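/- GENERATED by mk_final_copies.py from the proof of the farm's unit `start_decoder.C11` (farm:start_decoder.C11.2: Lemmas.lean) as the
   re-elaboration sweep compiled it — do not edit. -/
import Asan.CheckWalk
import Vorbis.Spec.Units.start_decoder_C11
import Vorbis.Spec.StartDecoderATest
import Vorbis.Spec.StartDecoderBTest

open X86 X86.User Asan Vorbis Vorbis.Spec Vorbis.Spec.StartDecoder

set_option maxRecDepth 4000
set_option maxHeartbeats 4000000

namespace Vorbis.Spec.start_decoder_C11

/-- The steady stack pointer of `Frame` in the form the walker computes with: relative to the entry state's `rsp`
(`Frame.rsp` says `addr g.R`, which `u_omega` / the walker's literal arithmetic do not see through). -/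
theorem rsp_form {u₀ : State} {g : Ghost} {pc : Word} {A : Arena × List Obj} {v : State} (h : Frame u₀ g pc A v) :
    v.reg .rsp = g.e.reg .rsp - 1480 := by
  have h1 := h.ra
  rw [h.rsp]
  unfold Ghost.R steady
  unfold Ghost.RA depth at *
  have h2 : 1480 ≤ (g.e.reg .rsp).toNat := by omega
  have h3 := addr_sub_lit (g.e.reg .rsp).toNat 1480 h2
  rw [addr_toNat] at h3
  exact h3.symm

/-- A frame slot `[R + k]` of the assertions (`mem.u64 (g.R + k)`) in the walker's spelling `e.rsp - d`, `k + d = 1480`. -/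
theorem slot_form {u₀ : State} {g : Ghost} {pc : Word} {A : Arena × List Obj} {v : State} (h : Frame u₀ g pc A v)
    (k d : Nat) (hk : k + d = 1480) : addr (g.R + k) = g.e.reg .rsp - UInt64.ofNat d := by
  have h1 := h.ra
  unfold Ghost.R steady
  unfold Ghost.RA depth at *
  have h2 : d ≤ (g.e.reg .rsp).toNat := by omega
  have h3 : (g.e.reg .rsp).toNat - 1480 + k = (g.e.reg .rsp).toNat - d := by omega
  rw [h3]
  unfold addr
  rw [UInt64.ofNat_sub h2, UInt64.ofNat_toNat]

/-- The windows of `*f` outside get_bits' footprint (`Reader.winsBits`): everything `SDw 3` reads besides `Bits`. -/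
def cfgWins : Wins := [(0, 48), (56, 84), (96, 136), (144, 1484), (1749, 1752), (1784, 1808)]

/-- **`SDw 3` over a change of memory** that leaves the shadow, the constant slots `[R+8, R+28H)` and the configuration windows of
`*f` alone, given `Bits f` for the new memory (a reader's post, or `store_off_obj`). -/
theorem sdw_transport {len : Nat} {A : Arena × List Obj} {Blk : Block → Prop} {Live : Nat → Prop} {mem mem' : Mem} {f R : Nat}
    (h : SDw len 3 A Blk Live mem f R) (hb : Bits Blk len mem' f) (hsh : ShadowUntouched mem mem')
    (hst : Mem.EqOn (R + 8) (R + 0x28) mem mem') (hR : R + 0x28 ≤ 2 ^ 64)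
    (he : ObjEq cfgWins mem f mem' f) : SDw len 3 A Blk Live mem' f R := by
  have ecbs : stb_vorbis.codebooks mem' f = stb_vorbis.codebooks mem f := by
    simp only [vacc, voff]
    exact he.u64 168 (by decide)
  refine
    { env := h.env.eqOn hsh
      frame := h.frame.frame hst hR
      arena := h.arena.transfer (he.sub (by decide))
      setups := h.setups
      bits := hb
      first := ?_
      discard0 := ?_
      header := fun hk => (h.header hk).transfer (he.sub (by decide))
      cb0 := fun hk => ⟨(h.cb0 hk).1.transfer (he.sub (by decide)) (fun _ _ hB => hB), ?_⟩
      rest := ?_ }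
  · have h1 := h.first
    simp only [vacc, voff] at h1 ⊢
    rw [he.u8 1749 (by decide)]
    exact h1
  · have h1 := h.discard0
    simp only [vacc, voff] at h1 ⊢
    rw [he.i32 1784 (by decide)]
    exact h1
  · rw [ecbs]
    exact (h.cb0 hk).2
  · have h1 := h.rest
    unfold RestZero restFrom at h1 ⊢
    simp only [voff] at h1 ⊢
    have e : (if 3 ≤ 2 then 160 else if 3 ≤ 5 then 176 else if 3 = 6 then 320 else if 3 = 7 then 464 else
        if 3 = 8 then 480 else if 3 = 9 then 868 else if 3 = 10 then 1400 else 1480) = 176 := by decide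
    rw [e] at h1 ⊢
    intro o ho1 ho2
    have hm : ((144, 1484) : Nat × Nat) ∈ cfgWins := by decide
    rw [he (144, 1484) hm o (by simp only []; omega) (by simp only []; omega)]
    exact h1 o ho1 ho2

/-- **CUR(i) over a change of memory that keeps every setup block of the arena** (a callee's footprint on the stack and in the
reader windows of `*f`: get_bits, float32_unpack, lookup1_values; a store into a TEMP block): the shadow, the frame slots
`[R+8, R+38H)` (the constants, the spills of `f` and `i`) and the configuration windows of `*f` read the same; `Bits f` for the new
memory is given; r14 is kept. -/
theorem cur_transport {g : Ghost} {i : Nat} {A2 A3 Ai : Arena} {A : Arena × List Obj} {v s : State}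
    (h : Cur g i A2 A3 Ai A v) (hr14 : s.reg .r14 = v.reg .r14)
    (hb : Bits (g.Blk A) g.len s.mem g.f) (hsh : ShadowUntouched v.mem s.mem)
    (hst : Mem.EqOn (g.R + 8) (g.R + 0x38) v.mem s.mem) (hR : g.R + 0x38 ≤ 2 ^ 64)
    (he : ObjEq cfgWins v.mem g.f s.mem g.f) (hk : AllKept A.1.Blk v.mem s.mem) : Cur g i A2 A3 Ai A s := by
  have ecbs : stb_vorbis.codebooks s.mem g.f = stb_vorbis.codebooks v.mem g.f := by
    simp only [vacc, voff]
    exact he.u64 168 (by decide)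
  have ecnt : stb_vorbis.codebook_count s.mem g.f = stb_vorbis.codebook_count v.mem g.f := by
    simp only [vacc, voff]
    exact he.i32 160 (by decide)
  have ecb : g.cb s.mem i = g.cb v.mem i := by
    unfold Ghost.cb
    simp only [stb_vorbis.codebooks_at]
    rw [ecbs]
  have hcb := h.ages.cbOK
  have hcbA : A.1.Blk (codebooksBlock v.mem g.f) := hcb.F2.mono h.ages.exti
  have hkcb := hk _ hcbA
  have hF1 := h.ages.F1
  refine
    { sd := sdw_transport h.sd hb hsh (hst.mono (Nat.le_refl _) (by omega)) (by omega) he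
      hand := h.hand
      ages := h.ages.frame_old (he.sub (by decide)) (fun B hB => hk B (hB.mono h.ages.exti))
      zf := ?_
      lt := ?_
      slot_f := ?_
      slot_i := ?_
      r14 := ?_ }
  · rw [ecbs, ecnt]
    have hlt := h.lt
    have hw := hkcb.inside
    have hsm := hkcb.same
    simp only [vblock] at hw hsm
    apply h.zf.same
    · apply Mem.EqOn.mono hsm
      · simp only [voff]
        omega
      · exact Nat.le_refl _
    · omega
    · exact hw
  · rw [ecnt]
    exact h.lt
  · rw [← h.slot_f]
    exact hst.u64 (g.R + 0x18) (by omega) (by omega) (by omega)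
  · rw [← h.slot_i]
    exact hst.u32 (g.R + 0x30) (by omega) (by omega) (by omega)
  · rw [hr14, ecb]
    exact h.r14

/-- What `InC11` says about the book under construction (memory level): K1 – K5, `lookup_type ∈ {1, 2}`, FIX 3, `multiplicands`
still NULL. (`lookup_values = 0` is dropped: the segment stores the field.) -/
structure Book11 (g : Ghost) (i : Nat) (Ai : Arena) (A : Arena × List Obj) (mem : Mem) : Prop where
  k : K15 (Since Ai A.1) mem (g.cb mem i)
  type_12 : Codebook.lookup_type mem (g.cb mem i) = 1 ∨ Codebook.lookup_type mem (g.cb mem i) = 2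
  prod_le : Codebook.entries mem (g.cb mem i) * Codebook.dimensions mem (g.cb mem i) ≤ 0x1FFFFFFF
  mu0 : Codebook.multiplicands mem (g.cb mem i) = 0

/-- The entry assertion gives the record. -/
theorem Book11.of_inC11 {u₀ : State} {g : Ghost} {i : Nat} {A2 A3 Ai : Arena} {A : Arena × List Obj} {v : State}
    (h : InC11 u₀ g i A2 A3 Ai A v) : Book11 g i Ai A v.mem :=
  ⟨h.k, h.type_12, h.prod_le, h.mu0⟩

/-- **The book under construction over a change of memory that keeps every setup block of the arena** (companion of
`cur_transport`): the struct `cb(i)` and its `sorted_values` block are setup blocks. -/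
theorem Book11.transport {g : Ghost} {i : Nat} {A2 A3 Ai : Arena} {A : Arena × List Obj} {v : State} {mem' : Mem}
    (h : Cur g i A2 A3 Ai A v) (hb : Book11 g i Ai A v.mem) (ecb : g.cb mem' i = g.cb v.mem i)
    (hk : AllKept A.1.Blk v.mem mem') : Book11 g i Ai A mem' := by
  have hcb := h.ages.cbOK
  have hcbA : A.1.Blk (codebooksBlock v.mem g.f) := hcb.F2.mono h.ages.exti
  have hks : (Codebook.block (g.cb v.mem i)).Kept v.mem mem' := hcb.cb_kept (hk _ hcbA) i h.lt
  have e : Codebook.SameFields v.mem mem' (g.cb v.mem i) := Codebook.SameFields.of_kept hks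
  obtain ⟨hk15, ht, hp, hm⟩ := hb
  refine ⟨?_, ?_, ?_, ?_⟩
  · rw [ecb]
    apply hk15.frame hks
    intro hse
    exact hk _ (hk15.k4.sv hse).1
  · rw [ecb, e.lookup_type]
    exact ht
  · rw [ecb, e.entries, e.dimensions]
    exact hp
  · rw [ecb, e.multiplicands]
    exact hm

/-- **Where `*f` is, seen from inside start_decoder**: above the text, inside the data space, and — it is an object of the CALLERS'
frames or a non-stack object — above the return-address slot or off the stack region. (`LiveIn.where_` with the function's own
shadow layer only gives `R ≤ f`, which does not separate `*f` from the saved registers `[R+598H, R+5D0H)`.) -/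
theorem obj_where {u₀ : State} {g : Ghost} {pc : Word} {A : Arena × List Obj} {v : State} (hf : Frame u₀ g pc A v)
    (hh : g.Hand A) :
    0x119d40 ≤ g.f ∧ g.f + 1808 ≤ 0xC00000 ∧ (g.RA + 8 ≤ g.f ∨ g.f + 1808 ≤ 0x700000 ∨ 0x800000 ≤ g.f) := by
  have hobj : LiveIn A.2 g.frames' g.f Off.sizeof.stb_vorbis := hh.obj.mono (sub_frames' g A)
  have hw := hobj.where_ hf.shadow hf.offText (by decide)
  simp only [Off.sizeof.stb_vorbis] at hw
  obtain ⟨hw1, hw2, _⟩ := hw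
  refine ⟨hw1, hw2, ?_⟩
  obtain ⟨o, ho, k1, k2⟩ := hh.obj
  simp only [Off.sizeof.stb_vorbis] at k2
  rcases List.mem_append.mp ho with hs | hoth
  · unfold stackObjs at hs
    obtain ⟨bF, hbF, hin⟩ := List.mem_flatMap.mp hs
    have hmem : bF ∈ g.frames' := List.mem_cons_of_mem _ hbF
    obtain ⟨a1, a2, _, _, _⟩ := hf.shadow.stack.active bF hmem
    have hg := FrameLayout.objsAt_gran a1 a2 hin
    have hc := hf.callers bF hbF
    have hra := hf.ra.1
    have : o.gLo = o.base / 8 := rfl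
    left
    omega
  · have := hf.shadow.off o hoth
    unfold OffStack at this
    omega

/-- A span that a callee of this segment other than the allocators may write: the stack below the steady stack pointer `R`, or
one of the reader windows of `*f` (`Reader.winsBits`; `error`'s window `[f+140, f+144)` lies in the third). -/
def OffArena (g : Ghost) (w : Span) : Prop :=
  (g.RA - 1888 ≤ w.lo ∧ w.hi ≤ g.R) ∨ (g.f + 48 ≤ w.lo ∧ w.hi ≤ g.f + 56) ∨ (g.f + 84 ≤ w.lo ∧ w.hi ≤ g.f + 96) ∨
    (g.f + 136 ≤ w.lo ∧ w.hi ≤ g.f + 144) ∨ (g.f + 1484 ≤ w.lo ∧ w.hi ≤ g.f + 1749) ∨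
    (g.f + 1752 ≤ w.lo ∧ w.hi ≤ g.f + 1784)

/-- `*f` does not meet the global `log2_4` (two different blocks of the function's block predicate). -/
theorem obj_off_log2 {len : Nat} {f : Nat} {A : Arena × List Obj} (hok : BlkOK (blk len f A)) :
    f + 1808 ≤ 0x120640 ∨ 0x120650 ≤ f := by
  have h1 : blk len f A (objBlock f) := runBlk_extra List.mem_cons_self
  have h2 : blk len f A ⟨0x120640, 16⟩ := by
    apply runBlk_extra
    simp only [fixedBlocks, globalBlocks, List.mem_cons, Block.mk.injEq, or_true, true_or]
  have hd := hok.disjoint h1 h2 (by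
    intro e
    have := congrArg Block.size e
    simp only [objBlock, Off.sizeof.stb_vorbis] at this
    omega)
  simp only [vblock, Off.sizeof.stb_vorbis] at hd
  omega

/-- **SH7 for `log2_4` over a footprint that misses the table** `[120640H, 120650H)`. -/
theorem log2_carry {mem mem' : Mem} {ws : List Span} (h : Log2_4In mem) (hs : Mem.SameExcept ws mem mem')
    (hd : ∀ w, w ∈ ws → 0x120650 ≤ w.lo ∨ w.hi ≤ 0x120640) : Log2_4In mem' := by
  intro j hj
  rw [← h j hj]
  have e : (UInt64.ofNat (Vorbis.Globals.log2_4.beg + j)).toNat = 0x120640 + j := by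
    show (addr (0x120640 + j)).toNat = _
    exact toNat_addr _ (by omega)
  apply hs.readLE
  · rw [e]
    omega
  · intro w hw
    rw [e]
    have := hd w hw
    omega

/-- **The assertion of segment C11 between its calls** (every state from 0x114bad up to the `setup_temp_malloc` of line 3890): the
common part `Frame` at the state's own `rip`, CUR(i), the book under construction, no temp block. -/
structure Mid11 (u₀ : State) (g : Ghost) (i : Nat) (A2 A3 Ai : Arena) (A : Arena × List Obj) (s : State) : Prop where
  fr : Frame u₀ g s.rip A s
  cur : Cur g i A2 A3 Ai A s
  book : Book11 g i Ai A s.mem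
  noTemps : A.1.temps = []

/-- The entry assertion of the segment is `Mid11`. -/
theorem Mid11.of_inC11 {u₀ : State} {g : Ghost} {i : Nat} {A2 A3 Ai : Arena} {A : Arena × List Obj} {v : State}
    (h : InC11 u₀ g i A2 A3 Ai A v) : Mid11 u₀ g i A2 A3 Ai A v := by
  refine ⟨?_, h.cur, Book11.of_inC11 h, h.noTemps⟩
  rw [h.frame.rip]
  exact h.frame

/-- **`Mid11` OVER A CALL** whose footprint is `OffArena` (get_bits, float32_unpack, lookup1_values, error) — and over the segment's own
pushes of return addresses: the walker's `SameExcept` from the state `v` with `Mid11` to the returned state `s`, the shadow untouched,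
`Bits f` of the new memory (the callee's post / `store_off_obj`), rsp and r14 as before, the code span and the ABI invariant of the
returned state. -/
theorem Mid11.call {u₀ : State} {g : Ghost} {i : Nat} {A2 A3 Ai : Arena} {A : Arena × List Obj} {v s : State}
    (h : Mid11 u₀ g i A2 A3 Ai A v) {ws : List Span} (hs : Mem.SameExcept ws v.mem s.mem) (hws : ∀ w, w ∈ ws → OffArena g w)
    (hb : Bits (g.Blk A) g.len s.mem g.f) (hsh : ShadowUntouched v.mem s.mem) (hrsp : s.reg .rsp = v.reg .rsp)
    (hr14 : s.reg .r14 = v.reg .r14) (hcode : CodeOK u₀ s.mem) (hinv : abiInv s) :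
    Mid11 u₀ g i A2 A3 Ai A s := by
  obtain ⟨hfr, hcur, hbook, hno⟩ := h
  obtain ⟨hw1, hw2, hw3⟩ := obj_where hfr hcur.hand
  obtain ⟨hra1, hra2, hra3⟩ := hfr.ra
  obtain ⟨hr1, hr2⟩ := hfr.r_eq
  simp only [depth, steady] at hra2 hr1
  have ha := hcur.sd.arena
  have hout := hcur.objOut
  simp only [Off.sizeof.stb_vorbis] at hout
  -- a range of the own frame at or above `R` reads the same
  have hstack : ∀ lo hi, g.R ≤ lo → hi ≤ g.RA + 8 → Mem.EqOn lo hi v.mem s.mem := by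
    intro lo hi h1 h2
    apply hs.eqOn
    intro w hw
    have := hws w hw
    unfold OffArena at this
    omega
  -- the configuration windows of `*f` read the same
  have he : ObjEq cfgWins v.mem g.f s.mem g.f := by
    apply ObjEq.of_sameExcept hs
    · intro w hw
      simp only [cfgWins, List.mem_cons, List.mem_nil_iff, or_false] at hw
      rcases hw with rfl | rfl | rfl | rfl | rfl | rfl <;> simp only [] <;> omega
    · intro w hw sp hsp
      have := hws sp hsp
      unfold OffArena at this
      simp only [cfgWins, List.mem_cons, List.mem_nil_iff, or_false] at hw
      rcases hw with rfl | rfl | rfl | rfl | rfl | rfl <;> simp only [] <;> omega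
  -- every setup block of the arena is kept
  have hk : AllKept A.1.Blk v.mem s.mem := by
    apply AllKept.of_sameExcept ha.blkOK hs
    intro B hB w hw
    have h1 := ha.blk_off_stack hB
    have h2 := arena_inside ha hB
    have := hws w hw
    unfold OffArena at this
    omega
  have ecb : g.cb s.mem i = g.cb v.mem i := by
    unfold Ghost.cb
    simp only [stb_vorbis.codebooks_at, vacc, voff]
    rw [he.u64 168 (by decide)]
  have hlog : Log2_4In s.mem := by
    apply log2_carry hfr.sh7 hs
    intro w hw
    have hol := obj_off_log2 hcur.sd.env.ok
    have := hws w hw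
    unfold OffArena at this
    omega
  have hcur' : Cur g i A2 A3 Ai A s :=
    cur_transport hcur hr14 hb hsh (hstack _ _ (by omega) (by omega)) (by omega) he hk
  refine ⟨?_, hcur', Book11.transport hcur hbook ecb hk, hno⟩
  have e8 := hstack (g.R + 8) (g.R + 16) (by omega) (by omega)
  have esv := hstack (g.R + 0x598) (g.R + 0x5d0) (by omega) (by omega)
  refine
    { entry := hfr.entry
      rip := rfl
      rsp := hrsp.trans hfr.rsp
      shadowIdx := (e8.u64 (g.R + 8) (by omega) (by omega) (by omega)).trans hfr.shadowIdx
      saved_rbx := (esv.u64 (g.R + 0x598) (by omega) (by omega) (by omega)).trans hfr.saved_rbx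
      saved_rbp := (esv.u64 (g.R + 0x5a0) (by omega) (by omega) (by omega)).trans hfr.saved_rbp
      saved_r12 := (esv.u64 (g.R + 0x5a8) (by omega) (by omega) (by omega)).trans hfr.saved_r12
      saved_r13 := (esv.u64 (g.R + 0x5b0) (by omega) (by omega) (by omega)).trans hfr.saved_r13
      saved_r14 := (esv.u64 (g.R + 0x5b8) (by omega) (by omega) (by omega)).trans hfr.saved_r14
      saved_r15 := (esv.u64 (g.R + 0x5c0) (by omega) (by omega) (by omega)).trans hfr.saved_r15
      saved_ra := (esv.u64 (g.R + 0x5c8) (by omega) (by omega) (by omega)).trans hfr.saved_ra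
      code := hcode
      inv := hinv
      shadow := hfr.shadow.untouched hsh
      offText := hfr.offText
      ext := hfr.ext
      callers := hfr.callers
      sh7 := hlog
      same := ?_ }
  apply hfr.same.trans
  apply hs.mono
  intro w hw a h1 h2
  have := hws w hw
  unfold OffArena at this
  have hobj : (g.f ≤ w.lo ∧ w.hi ≤ g.f + 1808) → ∃ w', w' ∈ footprint g ∧ w'.lo ≤ a ∧ a < w'.hi := by
    intro hin
    refine ⟨(objBlock (g.e.reg .rdi).toNat).span, List.mem_cons_of_mem _ List.mem_cons_self, ?_, ?_⟩
    · show g.f ≤ a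
      omega
    · show a < g.f + Off.sizeof.stb_vorbis
      simp only [Off.sizeof.stb_vorbis]
      omega
  rcases this with h0 | h0 | h0 | h0 | h0 | h0
  · refine ⟨⟨g.RA - depth, g.RA⟩, List.mem_cons_self, ?_, ?_⟩
    · show g.RA - depth ≤ a
      simp only [depth]
      omega
    · show a < g.RA
      omega
  · exact hobj (by omega)
  · exact hobj (by omega)
  · exact hobj (by omega)
  · exact hobj (by omega)
  · exact hobj (by omega)

/-- **The struct `cb(i)` in two memories that differ only in the fields segment C11 stores**: everything reads the same but
`minimum_value`, `delta_value`, `value_bits` (`[c+10H, c+19H)`), `sequence_p` (byte 1AH) and `lookup_values` (`[c+1CH, c+20H)`).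
(`Codebook.SameFields` — what `K15.frame` asks — is false over such a store.) -/
structure SameK (mem mem' : Mem) (c : Nat) : Prop where
  lo : Mem.EqOn c (c + 0x10) mem mem'
  lt : Mem.EqOn (c + 0x19) (c + 0x1a) mem mem'
  sp : Mem.EqOn (c + 0x1b) (c + 0x1c) mem mem'
  hi : Mem.EqOn (c + 0x20) (c + 2120) mem mem'
  wrap : c + 2120 ≤ 2 ^ 64

/-- One store of the walker inside the three field ranges gives `SameK`. -/
theorem SameK.of_writeLE (mem : Mem) (c b k x : Nat) (hc : c + 2120 ≤ 2 ^ 64)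
    (hin : (c + 0x10 ≤ b ∧ b + k ≤ c + 0x19) ∨ (c + 0x1a ≤ b ∧ b + k ≤ c + 0x1b) ∨ (c + 0x1c ≤ b ∧ b + k ≤ c + 0x20)) :
    SameK mem (mem.writeLE (addr b) k x) c := by
  have hb : (addr b).toNat = b := toNat_addr b (by omega)
  refine ⟨?_, ?_, ?_, ?_, hc⟩
  · exact Mem.eqOn_writeLE mem (addr b) k x c 0x10 (by omega) (by omega)
  · exact Mem.eqOn_writeLE mem (addr b) k x (c + 0x19) 1 (by omega) (by omega)
  · exact Mem.eqOn_writeLE mem (addr b) k x (c + 0x1b) 1 (by omega) (by omega)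
  · have e := Mem.eqOn_writeLE mem (addr b) k x (c + 0x20) 2088 (by omega) (by omega)
    exact e

/-- **K1 – K5 OF THE BOOK UNDER CONSTRUCTION OVER A STORE INTO ONE OF ITS OWN FIELDS** (the lemma the header of
Vorbis/Spec/StartDecoderA.lean announces as `K15.store_book`): K1 – K5 read `dimensions`, `entries`, `codeword_lengths`, `sparse`,
`codewords`, `fast_huffman`, `sorted_codewords`, `sorted_values`, `sorted_entries` and the `sorted_values` block — none of which
the store changes. -/
theorem k15_sameK {Blk : Block → Prop} {mem mem' : Mem} {c : Nat} (h : K15 Blk mem c) (e : SameK mem mem' c)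
    (hv : 1 ≤ Codebook.sorted_entries mem c → (Codebook.svBlock mem c).Kept mem mem') : K15 Blk mem' c := by
  obtain ⟨elo, elt, esp, ehi, hw⟩ := e
  have e_dim : Codebook.dimensions mem' c = Codebook.dimensions mem c := by
    simp only [vacc, voff]
    exact elo.i32 _ (by omega) (by omega) (by omega)
  have e_ent : Codebook.entries mem' c = Codebook.entries mem c := by
    simp only [vacc, voff]
    exact elo.i32 _ (by omega) (by omega) (by omega)
  have e_cl : Codebook.codeword_lengths mem' c = Codebook.codeword_lengths mem c := by
    simp only [vacc, voff]
    exact elo.u64 _ (by omega) (by omega) (by omega)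
  have e_sp : Codebook.sparse mem' c = Codebook.sparse mem c := by
    simp only [vacc, voff]
    exact esp.u8 _ (by omega) (by omega) (by omega)
  have e_cw : Codebook.codewords mem' c = Codebook.codewords mem c := by
    simp only [vacc, voff]
    exact ehi.u64 _ (by omega) (by omega) (by omega)
  have e_fh : ∀ k, k < 1024 → Codebook.fast_huffman mem' c k = Codebook.fast_huffman mem c k := by
    intro k hk
    simp only [vacc, voff]
    exact ehi.i16 _ (by omega) (by omega) (by omega)
  have e_sc : Codebook.sorted_codewords mem' c = Codebook.sorted_codewords mem c := by
    simp only [vacc, voff]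
    exact ehi.u64 _ (by omega) (by omega) (by omega)
  have e_sv : Codebook.sorted_values mem' c = Codebook.sorted_values mem c := by
    simp only [vacc, voff]
    exact ehi.u64 _ (by omega) (by omega) (by omega)
  have e_se : Codebook.sorted_entries mem' c = Codebook.sorted_entries mem c := by
    simp only [vacc, voff]
    exact ehi.i32 _ (by omega) (by omega) (by omega)
  have e_N : Codebook.N mem' c = Codebook.N mem c := by
    unfold Codebook.N
    rw [e_sp, e_ent, e_se]
  obtain ⟨k1, k2, k3, k4, k4c, k5⟩ := h
  refine ⟨?_, ?_, ?_, ?_, ?_, ?_⟩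
  · -- K1
    refine ⟨?_, ?_, ?_, ?_⟩
    · rw [e_dim]
      exact k1.dim_pos
    · rw [e_dim]
      exact k1.dim_le
    · rw [e_ent]
      exact k1.ent_nonneg
    · rw [e_ent]
      exact k1.ent_lt
  · -- K2
    refine ⟨?_, ?_, ?_, ?_, ?_⟩
    · rw [e_sp]
      exact k2.sparse_01
    · rw [e_se]
      exact k2.se_nonneg
    · rw [e_se, e_ent]
      exact k2.se_le
    · rw [e_sp, e_se]
      exact k2.sparse_pos
    · rw [e_sp, e_se, e_ent]
      exact k2.sparse_quarter
  · -- K3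
    refine ⟨?_, ?_⟩
    · intro hs
      rw [e_sp] at hs
      have k := k3.dense hs
      refine ⟨?_, ?_⟩
      · rw [e_cl, e_ent]
        exact k.lengths
      · rw [e_cw, e_ent]
        exact k.codewords
    · intro hs
      rw [e_sp] at hs
      have k := k3.sparse hs
      refine ⟨?_, ?_⟩
      · rw [e_cl, e_se]
        exact k.lengths
      · rw [e_cw]
        exact k.codewords_null
  · -- K4
    refine ⟨?_, ?_, ?_, ?_⟩
    · rw [e_se, e_sc]
      exact k4.sc
    · rw [e_se, e_sv]
      exact k4.sv
    · rw [e_se, e_sv]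
      intro hse
      have hkv := hv hse
      have e4 : mem'.i32 (Codebook.sorted_values mem c - 4) = mem.i32 (Codebook.sorted_values mem c - 4) := by
        apply hkv.i32
        · exact Nat.le_refl _
        · simp only []
          omega
      rw [e4]
      exact k4.sentinel hse
    · rw [e_se, e_sc, e_sv]
      exact k4.null
  · -- K4c
    intro x hx
    rw [e_se] at hx
    have hse : 1 ≤ Codebook.sorted_entries mem c := by omega
    have hkv := hv hse
    have ex : mem'.i32 (Codebook.sorted_values_at mem c x) = mem.i32 (Codebook.sorted_values_at mem c x) := by
      simp only [Codebook.sorted_values_at]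
      apply hkv.i32
      · simp only []
        omega
      · simp only []
        omega
    have eat : Codebook.sorted_values_at mem' c x = Codebook.sorted_values_at mem c x := by
      simp only [Codebook.sorted_values_at, e_sv]
    rw [eat, ex, e_ent]
    exact k4c x hx
  · -- K5
    intro k hk
    rw [e_fh k hk, e_N]
    exact k5 k hk

/-- **`Mid11` OVER A STORE INTO A FIELD OF THE BOOK UNDER CONSTRUCTION** (`minimum_value`, `delta_value`, `value_bits`, `sequence_p`,
`lookup_values`: the five field stores of the segment): `s.mem` is `v.mem` with `k` bytes stored at `b` inside
`[c+10H, c+19H)`, `[c+1AH, c+1BH)` or `[c+1CH, c+20H)`, `c = cb(i)`. -/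
theorem Mid11.store_field {u₀ : State} {g : Ghost} {i : Nat} {A2 A3 Ai : Arena} {A : Arena × List Obj} {v s : State}
    (h : Mid11 u₀ g i A2 A3 Ai A v) {b k x : Nat} (hm : s.mem = v.mem.writeLE (addr b) k x)
    (hin : (g.cb v.mem i + 0x10 ≤ b ∧ b + k ≤ g.cb v.mem i + 0x19) ∨ (g.cb v.mem i + 0x1a ≤ b ∧ b + k ≤ g.cb v.mem i + 0x1b) ∨
      (g.cb v.mem i + 0x1c ≤ b ∧ b + k ≤ g.cb v.mem i + 0x20))
    (hrsp : s.reg .rsp = v.reg .rsp) (hr14 : s.reg .r14 = v.reg .r14) (hcode : CodeOK u₀ s.mem) (hinv : abiInv s) :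
    Mid11 u₀ g i A2 A3 Ai A s := by
  obtain ⟨hfr, hcur, hbook, hno⟩ := h
  obtain ⟨hw1, hw2, hw3⟩ := obj_where hfr hcur.hand
  obtain ⟨hra1, hra2, hra3⟩ := hfr.ra
  obtain ⟨hr1, hr2⟩ := hfr.r_eq
  simp only [depth, steady] at hra2 hr1
  have ha := hcur.sd.arena
  have hout := hcur.objOut
  simp only [Off.sizeof.stb_vorbis] at hout
  -- where the struct is: inside the codebooks block, a setup block of the arena
  have hcb := hcur.ages.cbOK
  have hcbA : A.1.Blk (codebooksBlock v.mem g.f) := hcb.F2.mono hcur.ages.exti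
  have hci := hcb.cb_in i hcur.lt
  have hstk := ha.blk_off_stack hcbA
  have hins := arena_inside ha hcbA
  have hbnd := ha.bounds
  have htxt := hcur.hand.arenaText
  have etxt : L.textHi = 0x119d40 := rfl
  have hc : g.cb v.mem i = stb_vorbis.codebooks_at v.mem g.f i := rfl
  simp only [vblock, voff] at hci hstk hins
  have hbk : b + k ≤ 0xC00000 := by omega
  have hb2 : (addr b).toNat = b := toNat_addr b (by omega)
  have hinB : (Codebook.block (g.cb v.mem i)).contains b k := by
    simp only [vblock, voff]
    omega
  -- a byte off the store reads the same
  have hrd : ∀ a : Word, (a.toNat < b ∨ b + k ≤ a.toNat) → s.mem.read a = v.mem.read a := by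
    intro a hd
    rw [hm]
    apply Mem.read_writeLE_disjoint_noWrap v.mem (addr b) k x a
    · unfold Mem.NoWrap
      omega
    · omega
  have hoff : ∀ lo hi, (hi ≤ b ∨ b + k ≤ lo) → Mem.EqOn lo hi v.mem s.mem := by
    intro lo hi hd a h1 h2
    apply hrd
    omega
  have hsh : ShadowUntouched v.mem s.mem := hoff _ _ (by omega)
  have hb' : Bits (g.Blk A) g.len s.mem g.f := by
    rw [hm]
    exact (Reader.store_off_obj hcur.sd.bits (addr b) k x (by omega) (by omega)).1.bits
  have he : ObjEq cfgWins v.mem g.f s.mem g.f := by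
    rw [hm]
    apply ObjEq.of_writeLE v.mem g.f (addr b) k x (by omega)
    · intro w hw
      simp only [cfgWins, List.mem_cons, List.mem_nil_iff, or_false] at hw
      rcases hw with rfl | rfl | rfl | rfl | rfl | rfl <;> simp only [] <;> omega
    · intro w hw
      simp only [cfgWins, List.mem_cons, List.mem_nil_iff, or_false] at hw
      rcases hw with rfl | rfl | rfl | rfl | rfl | rfl <;> simp only [] <;> omega
  have ecbs : stb_vorbis.codebooks s.mem g.f = stb_vorbis.codebooks v.mem g.f := by
    simp only [vacc, voff]
    exact he.u64 168 (by decide)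
  have ecnt : stb_vorbis.codebook_count s.mem g.f = stb_vorbis.codebook_count v.mem g.f := by
    simp only [vacc, voff]
    exact he.i32 160 (by decide)
  have ecb : g.cb s.mem i = g.cb v.mem i := by
    unfold Ghost.cb
    simp only [stb_vorbis.codebooks_at]
    rw [ecbs]
  have hages : BookTrans A2 A3 Ai A.1 s.mem g.f i := by
    rw [hm]
    exact hcur.store_book (by simp only [Off.sizeof.stb_vorbis]; omega) x hinB
  have hF1 := hcur.ages.F1
  have hlt := hcur.lt
  have hcur' : Cur g i A2 A3 Ai A s := by
    refine
      { sd := sdw_transport hcur.sd hb' hsh (hoff _ _ (by omega)) (by omega) he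
        hand := hcur.hand
        ages := hages
        zf := ?_
        lt := ?_
        slot_f := ?_
        slot_i := ?_
        r14 := ?_ }
    · rw [ecbs, ecnt]
      apply hcur.zf.same
      · apply hoff
        simp only [stb_vorbis.codebooks_at, voff] at hc
        simp only [voff]
        omega
      · omega
      · simp only [voff]
        omega
    · rw [ecnt]
      exact hcur.lt
    · rw [← hcur.slot_f]
      exact (hoff (g.R + 0x18) (g.R + 0x20) (by omega)).u64 (g.R + 0x18) (by omega) (by omega) (by omega)
    · rw [← hcur.slot_i]
      exact (hoff (g.R + 0x30) (g.R + 0x34) (by omega)).u32 (g.R + 0x30) (by omega) (by omega) (by omega)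
    · rw [hr14, ecb]
      exact hcur.r14
  have hsk : SameK v.mem s.mem (g.cb v.mem i) := by
    rw [hm]
    exact SameK.of_writeLE v.mem _ b k x (by omega) hin
  have hbook' : Book11 g i Ai A s.mem := by
    obtain ⟨hk15, ht, hp, hmu⟩ := hbook
    obtain ⟨elo, elt, esp, ehi, hwr⟩ := hsk
    refine ⟨?_, ?_, ?_, ?_⟩
    · rw [ecb]
      apply k15_sameK hk15 ⟨elo, elt, esp, ehi, hwr⟩
      intro hse
      rw [hm]
      exact hcur.young_kept (hk15.k4.sv hse) x hinB
    · rw [ecb]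
      have e : Codebook.lookup_type s.mem (g.cb v.mem i) = Codebook.lookup_type v.mem (g.cb v.mem i) := by
        simp only [vacc, voff]
        exact elt.u8 _ (by omega) (by omega) (by omega)
      rw [e]
      exact ht
    · rw [ecb]
      have e1 : Codebook.entries s.mem (g.cb v.mem i) = Codebook.entries v.mem (g.cb v.mem i) := by
        simp only [vacc, voff]
        exact elo.i32 _ (by omega) (by omega) (by omega)
      have e2 : Codebook.dimensions s.mem (g.cb v.mem i) = Codebook.dimensions v.mem (g.cb v.mem i) := by
        simp only [vacc, voff]
        exact elo.i32 _ (by omega) (by omega) (by omega)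
      rw [e1, e2]
      exact hp
    · rw [ecb]
      have e : Codebook.multiplicands s.mem (g.cb v.mem i) = Codebook.multiplicands v.mem (g.cb v.mem i) := by
        simp only [vacc, voff]
        exact ehi.u64 _ (by omega) (by omega) (by omega)
      rw [e]
      exact hmu
  have hlog : Log2_4In s.mem := by
    have hs1 : Mem.SameExcept [⟨b, b + k⟩] v.mem s.mem := by
      intro a ha
      apply hrd
      have := ha ⟨b, b + k⟩ List.mem_cons_self
      simp only [] at this
      omega
    apply log2_carry hfr.sh7 hs1
    intro w hw
    have e1 : w = ⟨b, b + k⟩ := List.mem_singleton.mp hw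
    subst e1
    have ho := hcur.hand.outside ⟨0x120640, 16⟩ (by
      simp only [fixedBlocks, globalBlocks, List.mem_cons, Block.mk.injEq, or_true, true_or])
    simp only [] at ho ⊢
    omega
  refine ⟨?_, hcur', hbook', hno⟩
  have e8 := hoff (g.R + 8) (g.R + 16) (by omega)
  have esv := hoff (g.R + 0x598) (g.R + 0x5d0) (by omega)
  refine
    { entry := hfr.entry
      rip := rfl
      rsp := hrsp.trans hfr.rsp
      shadowIdx := (e8.u64 (g.R + 8) (by omega) (by omega) (by omega)).trans hfr.shadowIdx
      saved_rbx := (esv.u64 (g.R + 0x598) (by omega) (by omega) (by omega)).trans hfr.saved_rbx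
      saved_rbp := (esv.u64 (g.R + 0x5a0) (by omega) (by omega) (by omega)).trans hfr.saved_rbp
      saved_r12 := (esv.u64 (g.R + 0x5a8) (by omega) (by omega) (by omega)).trans hfr.saved_r12
      saved_r13 := (esv.u64 (g.R + 0x5b0) (by omega) (by omega) (by omega)).trans hfr.saved_r13
      saved_r14 := (esv.u64 (g.R + 0x5b8) (by omega) (by omega) (by omega)).trans hfr.saved_r14
      saved_r15 := (esv.u64 (g.R + 0x5c0) (by omega) (by omega) (by omega)).trans hfr.saved_r15
      saved_ra := (esv.u64 (g.R + 0x5c8) (by omega) (by omega) (by omega)).trans hfr.saved_ra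
      code := hcode
      inv := hinv
      shadow := hfr.shadow.untouched hsh
      offText := hfr.offText
      ext := hfr.ext
      callers := hfr.callers
      sh7 := hlog
      same := ?_ }
  apply hfr.same.trans
  have hs1 : Mem.SameExcept [⟨b, b + k⟩] v.mem s.mem := by
    intro a ha
    apply hrd
    have := ha ⟨b, b + k⟩ List.mem_cons_self
    simp only [] at this
    omega
  apply hs1.mono
  intro w hw a h1 h2
  have e1 : w = ⟨b, b + k⟩ := List.mem_singleton.mp hw
  subst e1
  simp only [] at h1 h2
  have eB := hfr.ext.B
  have eL := hfr.ext.L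
  refine ⟨⟨g.A0.1.B, g.A0.1.B + g.A0.1.L⟩, ?_, ?_, ?_⟩
  · unfold footprint writes
    simp only [List.mem_cons, true_or, or_true]
  · show g.A0.1.B ≤ a
    omega
  · show a < g.A0.1.B + g.A0.1.L
    omega

/-- **The state right after a `call` from a state with `Mid11`** (the return address pushed at `[R − 8]`): the shadow clause of any
callee's precondition, and `Bits f` for the memory with the pushed word. -/
theorem call_pre {u₀ : State} {g : Ghost} {i : Nat} {A2 A3 Ai : Arena} {A : Arena × List Obj} {v s : State}
    (h : Mid11 u₀ g i A2 A3 Ai A v) {x : Nat} (hm : s.mem = v.mem.writeLE (g.e.reg .rsp - 1488) 8 x)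
    (hrsp : s.reg .rsp = g.e.reg .rsp - 1488) :
    ShadowPre A.2 g.frames' s ∧ Bits (g.Blk A) g.len s.mem g.f ∧ ShadowUntouched v.mem s.mem := by
  obtain ⟨hw1, hw2, hw3⟩ := obj_where h.fr h.cur.hand
  obtain ⟨hra1, hra2, hra3⟩ := h.fr.ra
  obtain ⟨hr1, hr2⟩ := h.fr.r_eq
  simp only [depth, steady] at hra2 hr1
  unfold Ghost.RA at hra1 hra2 hra3 hr1 hw3
  have e : (g.e.reg .rsp - 1488).toNat = (g.e.reg .rsp).toNat - 1488 := by u_omega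
  have hun : ShadowUntouched v.mem s.mem := by
    rw [hm]
    exact Mem.eqOn_writeLE v.mem _ 8 x 0xC00000 0x200000 (by omega) (by omega)
  refine ⟨shadowPre_call h.fr ?_ hun, ?_, hun⟩
  · rw [hrsp, e]
    omega
  · rw [hm]
    exact (Reader.store_off_obj h.cur.sd.bits _ 8 x (by omega) (by omega)).1.bits

/-- `Bits f` over a footprint that misses `*f` (an unprotected callee's own frame: float32_unpack, lookup1_values). -/
theorem bits_off {Blk : Block → Prop} {len : Nat} {mem mem' : Mem} {f : Nat} {ws : List Span} (h : Bits Blk len mem f)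
    (hs : Mem.SameExcept ws mem mem') (hd : ∀ w, w ∈ ws → f + 1808 ≤ w.lo ∨ w.hi ≤ f) : Bits Blk len mem' f := by
  apply h.frame_fields
  apply Bits.SameFields.of_sameExcept hs
  · intro w hw
    have := hd w hw
    omega
  · intro w hw
    have := hd w hw
    omega
  · intro w hw
    have := hd w hw
    omega
  · intro w hw
    have := hd w hw
    omega

/-- **The assertion at a cut point of segment C11 before the `setup_temp_malloc`**: `Mid11`, the program counter, r15 = f. -/
structure AtPt (u₀ : State) (g : Ghost) (i : Nat) (A2 A3 Ai : Arena) (A : Arena × List Obj) (pc : Word) (s : State) : Prop where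
  mid : Mid11 u₀ g i A2 A3 Ai A s
  rip : s.rip = pc
  r15 : s.reg .r15 = addr g.f

/-- The hypotheses every leg shares: the layout, the microarchitecture, the function's bytes. -/
structure Env0 (Lay : Layout) (μ : Microarch) (u₀ : State) : Prop where
  lay : Lay.hi = 0x1000000
  micro : UserX.MicroOK μ
  code : HasCodeNat Lay u₀ Vorbis.L.start_decoder.entry Vorbis.Code.code_start_decoder.nat Vorbis.L.start_decoder.size

/-- **Leg A, 0x114bad → 0x114bc6** (`cut149` → `cut151`; C line 3878 up to the return of `float32_unpack(get_bits(f, 32))`). -/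
theorem legA {Lay : Layout} {μ : Microarch} {u₀ : State} (henv : Env0 Lay μ u₀)
    (h_get_bits : ∀ (others : List Obj) (frames : List (Nat × FrameLayout)) (Blk : Block → Prop) (len : Nat),
      Calls Lay μ Vorbis.WayInv (Vorbis.conv u₀) Vorbis.L.get_bits.entry (Vorbis.Spec.get_bits.spec others frames Blk len))
    (h_f32 : ∀ (others : List Obj) (frames : List (Nat × FrameLayout)),
      Calls Lay μ Vorbis.WayInv (Vorbis.conv u₀) Vorbis.L.float32_unpack.entry (Vorbis.Spec.float32_unpack.spec others frames))
    (g : Ghost) (i : Nat) (A2 A3 Ai : Arena) (A : Arena × List Obj) (v : State) (h : InC11 u₀ g i A2 A3 Ai A v) :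
    ReachVia Lay μ WayInv v (fun w => AtPt u₀ g i A2 A3 Ai A Vorbis.L.start_decoder.cut151 w) := by
  obtain ⟨hLay, hμ, hcode⟩ := henv
  have hmid := Mid11.of_inC11 h
  have he := h.frame.entry
  v_entry he
  have w_rip := h.frame.rip
  have c_rsp := rsp_form h.frame
  have c_r14 := h.cur.r14
  have w_eq : Mem.EqOn Vorbis.L.textLo Vorbis.L.textHi u₀.mem v.mem := h.frame.code
  have hdf : v.flags .df = false := (show abiInv _ from h.frame.inv).1
  have hmx : v.mxcsr &&& 0x1F80 = 0x1F80 := (show abiInv _ from h.frame.inv).2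
  have hsse := Vorbis.sseOK_of_abiInv h.frame.inv
  have sf : v.mem.readLE (g.e.reg .rsp - 1456) 8 = g.f := by
    have e := slot_form h.frame 24 1456 (by omega)
    have hs := h.cur.slot_f
    unfold Mem.u64 at hs
    rw [e] at hs
    exact hs
  have hgb := h_get_bits A.2 g.frames' (g.Blk A) g.len
  have hfu := h_f32 A.2 g.frames'
  simp only [depth] at he_room he_stack
  have hRA := h.frame.r_eq
  have hR : g.R = (g.e.reg .rsp).toNat - 1480 := rfl
  obtain ⟨hw1, hw2, hw3⟩ := obj_where h.frame h.cur.hand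
  unfold Ghost.RA at hw3
  have hfdef : g.f = (g.e.reg .rdi).toNat := rfl
  u_walk hcode [hμ.vendor] until [Vorbis.L.start_decoder.cut150] span [Vorbis.L.textLo, Vorbis.L.textHi] side (v_side)
  · v_inv
  · -- pre of get_bits(f, 32)
    obtain ⟨hsh, hb, hun⟩ := call_pre hmid w_mem w_rsp
    have hrdi : (s_114bba.reg .rdi).toNat = g.f := by
      rw [w_rdi]
      unfold Ghost.f
      rw [UInt64.ofNat_toNat]
    refine ⟨⟨hsh, ?_, ?_⟩, ?_⟩
    · rw [hrdi]
      exact readerEnv h.cur.hand h.cur.sd.env.live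
    · rw [hrdi]
      exact hb
    · rw [bitsArg_def, w_rsi]
      decide
  · v_after_call w_rsp_114bba w_mem_114bba
    have c_rdi : s_114bba.reg .rdi = g.e.reg .rdi := by
      rw [w_rdi_114bba]
      unfold Ghost.f
      rw [UInt64.ofNat_toNat]
    simp only [c_rdi] at w_same
    obtain ⟨_, _, hun0⟩ := call_pre hmid w_mem_114bba w_rsp_114bba
    have hun : ShadowUntouched v.mem s_114bbar.mem := Mem.EqOn.trans hun0 w_post.untouched
    have hsame : Mem.SameExcept
        [⟨(g.e.reg .rsp).toNat - 1840, (g.e.reg .rsp).toNat - 1480⟩,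
         ⟨(g.e.reg .rdi).toNat + 48, (g.e.reg .rdi).toNat + 56⟩, ⟨(g.e.reg .rdi).toNat + 84, (g.e.reg .rdi).toNat + 96⟩,
         ⟨(g.e.reg .rdi).toNat + 136, (g.e.reg .rdi).toNat + 144⟩, ⟨(g.e.reg .rdi).toNat + 1484, (g.e.reg .rdi).toNat + 1749⟩,
         ⟨(g.e.reg .rdi).toNat + 1752, (g.e.reg .rdi).toNat + 1784⟩] v.mem s_114bbar.mem := by
      u_same
    have hb1 : Bits (g.Blk A) g.len s_114bbar.mem g.f := by
      have hb := w_post.bits.bits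
      rw [c_rdi] at hb
      exact hb
    have hmid1 : Mid11 u₀ g i A2 A3 Ai A s_114bbar := by
      refine hmid.call hsame ?_ hb1 hun (w_rsp.trans c_rsp.symm) ?_ w_eq w_inv
      · intro w hw
        unfold OffArena Ghost.RA
        simp only [List.mem_cons, List.mem_nil_iff, or_false] at hw
        rcases hw with rfl | rfl | rfl | rfl | rfl | rfl <;> simp only [] <;> omega
      · exact w_kept.get .r14 rfl
    -- from here on the state after the first call is the base: `Mid11` holds there
    obtain ⟨z, w_rax⟩ : ∃ z, s_114bbar.reg .rax = z := ⟨_, rfl⟩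
    have c_r14' : s_114bbar.reg .r14 = addr (g.cb v.mem i) := (w_kept.get .r14 rfl).trans c_r14
    have c_rsp1 : s_114bbar.reg .rsp = g.e.reg .rsp - 1480 := w_rsp
    have c_r14v : s_114bbar.reg .r14 = v.reg .r14 := w_kept.get .r14 rfl
    have c_r15 : s_114bbar.reg .r15 = addr g.f := w_r15
    clear hsame w_same w_post hun hun0 hb1 c_rdi w_mem_114bba w_kept_114bba w_rdi_114bba w_r15_114bba w_rsi_114bba
    clear w_rsp_114bba w_mxcsr_114bba w_has_114bba sf
    u_walk hcode [hμ.vendor] until [Vorbis.L.start_decoder.cut151] span [Vorbis.L.textLo, Vorbis.L.textHi] side (v_side)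
    · v_inv
    · -- pre of float32_unpack
      exact (call_pre hmid1 w_mem w_rsp).1
    · v_after_call w_rsp_114bc1 w_mem_114bc1
      obtain ⟨_, _, hun0⟩ := call_pre hmid1 w_mem_114bc1 w_rsp_114bc1
      have hun : ShadowUntouched s_114bbar.mem s_114bc1r.mem := Mem.EqOn.trans hun0 w_post
      have hsame : Mem.SameExcept [⟨(g.e.reg .rsp).toNat - 1840, (g.e.reg .rsp).toNat - 1480⟩]
          s_114bbar.mem s_114bc1r.mem := by
        u_same
      have hws : ∀ w, w ∈ [(⟨(g.e.reg .rsp).toNat - 1840, (g.e.reg .rsp).toNat - 1480⟩ : Span)] → OffArena g w := by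
        intro w hw
        unfold OffArena Ghost.RA
        have e1 := List.mem_singleton.mp hw
        subst e1
        simp only []
        omega
      have hb2 : Bits (g.Blk A) g.len s_114bc1r.mem g.f := by
        apply bits_off hmid1.cur.sd.bits hsame
        intro w hw
        have e1 := List.mem_singleton.mp hw
        subst e1
        simp only []
        omega
      have hmid2 : Mid11 u₀ g i A2 A3 Ai A s_114bc1r :=
        hmid1.call hsame hws hb2 hun (w_rsp.trans c_rsp1.symm) ((w_kept.get .r14 rfl).trans c_r14v.symm) w_eq w_inv
      refine ReachVia.done ⟨hmid2, w_rip, ?_⟩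
      exact w_r15

/-- **A check of `n` bytes at offset `off` of the struct `cb(i)`** (the 17 check sites of the segment but the `mults[j]` store): the
struct lies in the codebooks block, a live object; the shadow is that of the state with `Mid11`. -/
theorem check_field {u₀ : State} {g : Ghost} {i : Nat} {A2 A3 Ai : Arena} {A : Arena × List Obj} {v : State} {mem' : Mem}
    (h : Mid11 u₀ g i A2 A3 Ai A v) (hun : ShadowUntouched v.mem mem') (off n : Nat) (hoff : off + n ≤ 2120) (hn : 1 ≤ n)
    {b : Word} (hb : b.toNat = g.cb v.mem i + off) : AccSmall n mem' b := by
  have hok := (h.cur.sd.cb0 (by omega)).1.ok (h.cur.sd.cb0 (by omega)).2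
  have hs := hok.site_cb_field h.cur.sd.env.live i h.cur.lt off n (by simp only [voff]; omega) hn rfl
  exact check_site h.fr.shadow hun hs hb

/-- Where the struct `cb(i)` is: in the data space (so `c + 2120` does not wrap), off the stack, off the text. -/
theorem cb_where {u₀ : State} {g : Ghost} {i : Nat} {A2 A3 Ai : Arena} {A : Arena × List Obj} {v : State}
    (h : Mid11 u₀ g i A2 A3 Ai A v) :
    0x119d40 ≤ g.cb v.mem i ∧ g.cb v.mem i + 2120 ≤ 0xC00000 ∧
      (g.cb v.mem i + 2120 ≤ 0x700000 ∨ 0x800000 ≤ g.cb v.mem i) := by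
  have ha := h.cur.sd.arena
  have hcb := h.cur.ages.cbOK
  have hcbA : A.1.Blk (codebooksBlock v.mem g.f) := hcb.F2.mono h.cur.ages.exti
  have hci := hcb.cb_in i h.cur.lt
  have hstk := ha.blk_off_stack hcbA
  have hins := arena_inside ha hcbA
  have hbnd := ha.bounds
  have htxt := h.cur.hand.arenaText
  have etxt : L.textHi = 0x119d40 := rfl
  have hc : g.cb v.mem i = stb_vorbis.codebooks_at v.mem g.f i := rfl
  simp only [vblock, voff] at hci hstk hins
  omega

/-- **`Mid11` over a word pushed at `[R − 8]`** (the return address of a check call, which the segment's next store lies above in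
the walker's `w_mem`): the state with the pushed word as its memory. -/
theorem Mid11.push {u₀ : State} {g : Ghost} {i : Nat} {A2 A3 Ai : Arena} {A : Arena × List Obj} {v : State}
    (h : Mid11 u₀ g i A2 A3 Ai A v) (y : Nat) :
    Mid11 u₀ g i A2 A3 Ai A { v with mem := v.mem.writeLE (g.e.reg .rsp - 1488) 8 y } := by
  obtain ⟨hra1, hra2, hra3⟩ := h.fr.ra
  obtain ⟨hr1, hr2⟩ := h.fr.r_eq
  simp only [depth, steady] at hra2 hr1
  obtain ⟨hw1, hw2, hw3⟩ := obj_where h.fr h.cur.hand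
  have e : (g.e.reg .rsp - 1488).toNat = g.RA - 1488 := by
    unfold Ghost.RA at *
    u_omega
  have hs : Mem.SameExcept [⟨g.RA - 1488, g.RA - 1480⟩] v.mem (v.mem.writeLE (g.e.reg .rsp - 1488) 8 y) := by
    apply Mem.SameExcept.writeLE
    · omega
    · refine ⟨_, List.mem_cons_self, ?_, ?_⟩
      · simp only []
        omega
      · simp only []
        omega
  have hws : ∀ w, w ∈ [(⟨g.RA - 1488, g.RA - 1480⟩ : Span)] → OffArena g w := by
    intro w hw
    have e1 := List.mem_singleton.mp hw
    subst e1
    unfold OffArena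
    simp only []
    omega
  have hsh : ShadowUntouched v.mem (v.mem.writeLE (g.e.reg .rsp - 1488) 8 y) :=
    Mem.eqOn_writeLE v.mem _ 8 y 0xC00000 0x200000 (by omega) (by omega)
  have hb : Bits (g.Blk A) g.len (v.mem.writeLE (g.e.reg .rsp - 1488) 8 y) g.f :=
    (Reader.store_off_obj h.cur.sd.bits _ 8 y (by omega) (by omega)).1.bits
  have hcode : CodeOK u₀ (v.mem.writeLE (g.e.reg .rsp - 1488) 8 y) := by
    have hc : Mem.EqOn Vorbis.L.textLo Vorbis.L.textHi u₀.mem v.mem := h.fr.code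
    have e2 := Mem.eqOn_writeLE v.mem (g.e.reg .rsp - 1488) 8 y Vorbis.L.textLo (Vorbis.L.textHi - Vorbis.L.textLo)
      (by omega) (by
        have : Vorbis.L.textLo + (Vorbis.L.textHi - Vorbis.L.textLo) = 0x119d40 := by decide
        omega)
    exact Mem.EqOn.trans hc e2
  exact h.call (s := { v with mem := v.mem.writeLE (g.e.reg .rsp - 1488) 8 y }) hs hws hb hsh rfl rfl hcode h.fr.inv

/-- **Leg B, 0x114bc6 → 0x114bd7** (`cut151` → the end of C line 3878): `movd ebx, xmm0`, the check of `c->minimum_value`, the store. -/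
theorem legB1 {Lay : Layout} {μ : Microarch} {u₀ : State} (henv : Env0 Lay μ u₀)
    (hst4 : Asan.SmallCheck Lay μ Vorbis.WayInv (Vorbis.CodeOK u₀) [.rax, .rcx, .rdx] 4 Vorbis.L.__asan_store4_noabort.entry)
    (g : Ghost) (i : Nat) (A2 A3 Ai : Arena) (A : Arena × List Obj) (v : State)
    (hat : AtPt u₀ g i A2 A3 Ai A Vorbis.L.start_decoder.cut151 v) :
    ReachVia Lay μ WayInv v (fun w => AtPt u₀ g i A2 A3 Ai A 0x114bd7 w) := by
  obtain ⟨hLay, hμ, hcode⟩ := henv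
  obtain ⟨hmid, hrip, c_r15⟩ := hat
  have he := hmid.fr.entry
  v_entry he
  have w_rip := hrip
  have c_rsp := rsp_form hmid.fr
  have c_r14 := hmid.cur.r14
  have w_eq : Mem.EqOn Vorbis.L.textLo Vorbis.L.textHi u₀.mem v.mem := hmid.fr.code
  have hdf : v.flags .df = false := (show abiInv _ from hmid.fr.inv).1
  have hmx : v.mxcsr &&& 0x1F80 = 0x1F80 := (show abiInv _ from hmid.fr.inv).2
  have hsse := Vorbis.sseOK_of_abiInv hmid.fr.inv
  simp only [depth] at he_room he_stack
  obtain ⟨hc1, hc2, hc3⟩ := cb_where hmid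
  obtain ⟨c, hc⟩ : ∃ c, g.cb v.mem i = c := ⟨_, rfl⟩
  rw [hc] at c_r14 hc1 hc2 hc3
  u_walk hcode [hμ.vendor] until [0x114bd7] span [Vorbis.L.textLo, Vorbis.L.textHi] side (v_side)
  · -- the check of `c->minimum_value`
    have hun : ShadowUntouched v.mem s_114bce.mem := by v_untouched
    refine check_field hmid hun 16 4 (by omega) (by omega) ?_
    rw [hc]
    simp only [vfield]
    exact toNat_addr _ (by omega)
  · have e : (addr c + 16).toNat = c + 16 := by
      simp only [vfield]
      exact toNat_addr _ (by omega)
    rw [e]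
    omega
  · -- `Mid11` after the store
    have hp := hmid.push (L.start_decoder.cut151 + 13).toNat
    obtain ⟨hp1, hp2, hp3⟩ := cb_where hp
    dsimp only at hp1 hp2 hp3
    have ec : g.cb (v.mem.writeLE (g.e.reg Reg.rsp - 1488) 8 (L.start_decoder.cut151 + 13).toNat) i = c := by
      have h1 := hp.cur.r14
      have h2 : addr (g.cb (v.mem.writeLE (g.e.reg Reg.rsp - 1488) 8 (L.start_decoder.cut151 + 13).toNat) i) = addr c :=
        h1.symm.trans c_r14
      exact addr_inj _ _ (by omega) (by omega) h2
    simp only [vfield] at w_mem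
    have hm : Mid11 u₀ g i A2 A3 Ai A s_114bd3 := by
      refine hp.store_field (b := c + 16) (k := 4) w_mem ?_ (w_rsp.trans c_rsp.symm) (w_kept.get .r14 rfl) w_eq ?_
      · left
        rw [ec]
        omega
      · refine ⟨?_, ?_⟩
        · rw [w_flags]
          exact w_df_114bce
        · rw [w_mxcsr]
          exact hmx
    refine ReachVia.done ⟨hm, w_rip, ?_⟩
    rw [w_kept.get .r15 rfl]
    exact c_r15

/-- **ERRSTUB(20) of line 3889, 0x114d58 → 0x113b22** (`mov rbp, [rsp+18H] ; mov esi, 14H ; mov rdi, rbp ; call error ; jmp ERR`):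
from `Mid11` to the common epilogue's entry assertion with eax = 0 (`Cur.failed`). The stubs of lines 3884 (0x114d41) and 3891
(0x114d6f) are the same five instructions. -/
theorem stub_3889 {Lay : Layout} {μ : Microarch} {u₀ : State} (henv : Env0 Lay μ u₀)
    (h_error : ∀ (others : List Obj) (frames : List (Nat × FrameLayout)),
      Calls Lay μ Vorbis.WayInv (Vorbis.conv u₀) Vorbis.L.error.entry (Vorbis.Spec.error.spec others frames))
    (g : Ghost) (i : Nat) (A2 A3 Ai : Arena) (A : Arena × List Obj) (v : State)
    (hmid : Mid11 u₀ g i A2 A3 Ai A v) (hrip : v.rip = 0x114d58) :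
    ReachVia Lay μ WayInv v (fun w => AtERR u₀ g w) := by
  obtain ⟨hLay, hμ, hcode⟩ := henv
  have he := hmid.fr.entry
  v_entry he
  have w_rip := hrip
  have c_rsp := rsp_form hmid.fr
  have w_eq : Mem.EqOn Vorbis.L.textLo Vorbis.L.textHi u₀.mem v.mem := hmid.fr.code
  have hdf : v.flags .df = false := (show abiInv _ from hmid.fr.inv).1
  have hmx : v.mxcsr &&& 0x1F80 = 0x1F80 := (show abiInv _ from hmid.fr.inv).2
  have hsse := Vorbis.sseOK_of_abiInv hmid.fr.inv
  have sf : v.mem.readLE (g.e.reg .rsp - 1456) 8 = g.f := by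
    have e := slot_form hmid.fr 24 1456 (by omega)
    have hs := hmid.cur.slot_f
    unfold Mem.u64 at hs
    rw [e] at hs
    exact hs
  have herr := h_error A.2 g.frames'
  simp only [depth] at he_room he_stack
  obtain ⟨hw1, hw2, hw3⟩ := obj_where hmid.fr hmid.cur.hand
  unfold Ghost.RA at hw3
  have hfdef : g.f = (g.e.reg .rdi).toNat := rfl
  have hR : g.R = (g.e.reg .rsp).toNat - 1480 := rfl
  u_walk hcode [hμ.vendor] until [Vorbis.L.start_decoder.cut4] span [Vorbis.L.textLo, Vorbis.L.textHi] side (v_side)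
  · v_inv
  · -- pre of error(f, 20)
    refine ⟨(call_pre hmid w_mem w_rsp).1, ?_⟩
    have hrdi : (s_114d65.reg .rdi).toNat = g.f := by
      rw [w_rdi]
      unfold Ghost.f
      rw [UInt64.ofNat_toNat]
    rw [hrdi]
    exact hmid.cur.hand.obj.mono (sub_frames' g A)
  · v_after_call w_rsp_114d65 w_mem_114d65
    have c_rdi : s_114d65.reg .rdi = g.e.reg .rdi := by
      rw [w_rdi_114d65]
      unfold Ghost.f
      rw [UInt64.ofNat_toNat]
    simp only [c_rdi, voff] at w_same
    obtain ⟨hrax, hunp, _⟩ := w_post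
    obtain ⟨_, _, hun0⟩ := call_pre hmid w_mem_114d65 w_rsp_114d65
    have hun : ShadowUntouched v.mem s_114d65r.mem := Mem.EqOn.trans hun0 hunp
    have hsame : Mem.SameExcept
        [⟨(g.e.reg .rsp).toNat - 1840, (g.e.reg .rsp).toNat - 1480⟩,
         ⟨(g.e.reg .rdi).toNat + 140, (g.e.reg .rdi).toNat + 144⟩] v.mem s_114d65r.mem := by
      u_same
    have hws : ∀ w, w ∈ [(⟨(g.e.reg .rsp).toNat - 1840, (g.e.reg .rsp).toNat - 1480⟩ : Span),
        ⟨(g.e.reg .rdi).toNat + 140, (g.e.reg .rdi).toNat + 144⟩] → OffArena g w := by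
      intro w hw
      unfold OffArena Ghost.RA
      simp only [List.mem_cons, List.mem_nil_iff, or_false] at hw
      rcases hw with rfl | rfl <;> simp only [] <;> omega
    have hb : Bits (g.Blk A) g.len s_114d65r.mem g.f := by
      apply hmid.cur.sd.bits.frame_fields
      apply Bits.SameFields.of_sameExcept hsame
      all_goals
        intro w hw
        simp only [List.mem_cons, List.mem_nil_iff, or_false] at hw
        rcases hw with rfl | rfl <;> simp only [] <;> omega
    have hmid1 : Mid11 u₀ g i A2 A3 Ai A s_114d65r :=
      hmid.call hsame hws hb hun (w_rsp.trans c_rsp.symm) (w_kept.get .r14 rfl) w_eq w_inv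
    have c_rax : s_114d65r.reg .rax = 0 := hrax
    clear hsame w_same hun hun0 hunp hb
    u_walk hcode [hμ.vendor] until [Vorbis.L.start_decoder.cut4] span [Vorbis.L.textLo, Vorbis.L.textHi] side (v_side)
    -- the common epilogue's entry: `Mid11` survives the `jmp`, eax = 0, SD.ERR from CUR(i)
    have hfr : Frame u₀ g pc_ERR A s_114d6a := by
      have h1 : Frame u₀ g s_114d65r.rip A s_114d65r := hmid1.fr
      exact
        { entry := h1.entry
          rip := w_rip
          rsp := by
            rw [w_rsp, ← c_rsp]
            exact hmid.fr.rsp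
          shadowIdx := by
            rw [w_mem]
            exact h1.shadowIdx
          saved_rbx := by
            rw [w_mem]
            exact h1.saved_rbx
          saved_rbp := by
            rw [w_mem]
            exact h1.saved_rbp
          saved_r12 := by
            rw [w_mem]
            exact h1.saved_r12
          saved_r13 := by
            rw [w_mem]
            exact h1.saved_r13
          saved_r14 := by
            rw [w_mem]
            exact h1.saved_r14
          saved_r15 := by
            rw [w_mem]
            exact h1.saved_r15
          saved_ra := by
            rw [w_mem]
            exact h1.saved_ra
          code := w_eq
          inv := by
            refine ⟨?_, ?_⟩
            · rw [w_flags]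
              exact w_df
            · rw [w_mxcsr]
              exact w_mx
          shadow := by
            rw [w_mem]
            exact h1.shadow
          offText := h1.offText
          ext := h1.ext
          callers := h1.callers
          sh7 := by
            rw [w_mem]
            exact h1.sh7
          same := by
            rw [w_mem]
            exact h1.same }
    refine ReachVia.done ⟨A, hfr, hmid1.cur.hand, Or.inl ⟨?_, ?_⟩⟩
    · rw [w_rax]
      rfl
    · rw [w_mem]
      exact hmid1.cur.failed

/-- **Leg B2, 0x114bd7 → 0x114beb** (`cut153`; C line 3879 up to the return of `float32_unpack(get_bits(f, 32))`): as leg A, but `f`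
is already in r15. -/
theorem legB2 {Lay : Layout} {μ : Microarch} {u₀ : State} (henv : Env0 Lay μ u₀)
    (h_get_bits : ∀ (others : List Obj) (frames : List (Nat × FrameLayout)) (Blk : Block → Prop) (len : Nat),
      Calls Lay μ Vorbis.WayInv (Vorbis.conv u₀) Vorbis.L.get_bits.entry (Vorbis.Spec.get_bits.spec others frames Blk len))
    (h_f32 : ∀ (others : List Obj) (frames : List (Nat × FrameLayout)),
      Calls Lay μ Vorbis.WayInv (Vorbis.conv u₀) Vorbis.L.float32_unpack.entry (Vorbis.Spec.float32_unpack.spec others frames))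
    (g : Ghost) (i : Nat) (A2 A3 Ai : Arena) (A : Arena × List Obj) (v : State)
    (hat : AtPt u₀ g i A2 A3 Ai A 0x114bd7 v) :
    ReachVia Lay μ WayInv v (fun w => AtPt u₀ g i A2 A3 Ai A Vorbis.L.start_decoder.cut153 w) := by
  obtain ⟨hLay, hμ, hcode⟩ := henv
  obtain ⟨hmid, hrip, c_r15⟩ := hat
  have he := hmid.fr.entry
  v_entry he
  have w_rip := hrip
  have c_rsp := rsp_form hmid.fr
  have w_eq : Mem.EqOn Vorbis.L.textLo Vorbis.L.textHi u₀.mem v.mem := hmid.fr.code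
  have hdf : v.flags .df = false := (show abiInv _ from hmid.fr.inv).1
  have hmx : v.mxcsr &&& 0x1F80 = 0x1F80 := (show abiInv _ from hmid.fr.inv).2
  have hsse := Vorbis.sseOK_of_abiInv hmid.fr.inv
  have hgb := h_get_bits A.2 g.frames' (g.Blk A) g.len
  have hfu := h_f32 A.2 g.frames'
  simp only [depth] at he_room he_stack
  have hR : g.R = (g.e.reg .rsp).toNat - 1480 := rfl
  obtain ⟨hw1, hw2, hw3⟩ := obj_where hmid.fr hmid.cur.hand
  unfold Ghost.RA at hw3
  have hfdef : g.f = (g.e.reg .rdi).toNat := rfl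
  u_walk hcode [hμ.vendor] until [Vorbis.L.start_decoder.cut152] span [Vorbis.L.textLo, Vorbis.L.textHi] side (v_side)
  · v_inv
  · -- pre of get_bits(f, 32)
    obtain ⟨hsh, hb, hun⟩ := call_pre hmid w_mem w_rsp
    have hrdi : (s_114bdf.reg .rdi).toNat = g.f := by
      rw [w_rdi]
      exact toNat_addr g.f (by omega)
    refine ⟨⟨hsh, ?_, ?_⟩, ?_⟩
    · rw [hrdi]
      exact readerEnv hmid.cur.hand hmid.cur.sd.env.live
    · rw [hrdi]
      exact hb
    · rw [bitsArg_def, w_rsi]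
      decide
  · v_after_call w_rsp_114bdf w_mem_114bdf
    have c_rdi : s_114bdf.reg .rdi = g.e.reg .rdi := by
      rw [w_rdi_114bdf]
      exact addr_toNat _
    simp only [c_rdi] at w_same
    obtain ⟨_, _, hun0⟩ := call_pre hmid w_mem_114bdf w_rsp_114bdf
    have hun : ShadowUntouched v.mem s_114bdfr.mem := Mem.EqOn.trans hun0 w_post.untouched
    have hsame : Mem.SameExcept
        [⟨(g.e.reg .rsp).toNat - 1840, (g.e.reg .rsp).toNat - 1480⟩,
         ⟨(g.e.reg .rdi).toNat + 48, (g.e.reg .rdi).toNat + 56⟩, ⟨(g.e.reg .rdi).toNat + 84, (g.e.reg .rdi).toNat + 96⟩,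
         ⟨(g.e.reg .rdi).toNat + 136, (g.e.reg .rdi).toNat + 144⟩, ⟨(g.e.reg .rdi).toNat + 1484, (g.e.reg .rdi).toNat + 1749⟩,
         ⟨(g.e.reg .rdi).toNat + 1752, (g.e.reg .rdi).toNat + 1784⟩] v.mem s_114bdfr.mem := by
      u_same
    have hb1 : Bits (g.Blk A) g.len s_114bdfr.mem g.f := by
      have hb := w_post.bits.bits
      rw [c_rdi] at hb
      exact hb
    have hmid1 : Mid11 u₀ g i A2 A3 Ai A s_114bdfr := by
      refine hmid.call hsame ?_ hb1 hun (w_rsp.trans c_rsp.symm) (w_kept.get .r14 rfl) w_eq w_inv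
      intro w hw
      unfold OffArena Ghost.RA
      simp only [List.mem_cons, List.mem_nil_iff, or_false] at hw
      rcases hw with rfl | rfl | rfl | rfl | rfl | rfl <;> simp only [] <;> omega
    -- from here on the state after the first call is the base: `Mid11` holds there
    obtain ⟨z, w_rax⟩ : ∃ z, s_114bdfr.reg .rax = z := ⟨_, rfl⟩
    have c_rsp1 : s_114bdfr.reg .rsp = g.e.reg .rsp - 1480 := w_rsp
    have c_r14v : s_114bdfr.reg .r14 = v.reg .r14 := w_kept.get .r14 rfl
    have c_r15' : s_114bdfr.reg .r15 = addr g.f := (w_kept.get .r15 rfl).trans c_r15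
    clear hsame w_same w_post hun hun0 hb1 c_rdi w_mem_114bdf w_kept_114bdf w_rdi_114bdf w_rsi_114bdf
    clear w_rsp_114bdf w_mxcsr_114bdf w_has_114bdf
    u_walk hcode [hμ.vendor] until [Vorbis.L.start_decoder.cut153] span [Vorbis.L.textLo, Vorbis.L.textHi] side (v_side)
    · v_inv
    · -- pre of float32_unpack
      exact (call_pre hmid1 w_mem w_rsp).1
    · v_after_call w_rsp_114be6 w_mem_114be6
      obtain ⟨_, _, hun0⟩ := call_pre hmid1 w_mem_114be6 w_rsp_114be6
      have hun : ShadowUntouched s_114bdfr.mem s_114be6r.mem := Mem.EqOn.trans hun0 w_post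
      have hsame : Mem.SameExcept [⟨(g.e.reg .rsp).toNat - 1840, (g.e.reg .rsp).toNat - 1480⟩]
          s_114bdfr.mem s_114be6r.mem := by
        u_same
      have hws : ∀ w, w ∈ [(⟨(g.e.reg .rsp).toNat - 1840, (g.e.reg .rsp).toNat - 1480⟩ : Span)] → OffArena g w := by
        intro w hw
        unfold OffArena Ghost.RA
        have e1 := List.mem_singleton.mp hw
        subst e1
        simp only []
        omega
      have hb2 : Bits (g.Blk A) g.len s_114be6r.mem g.f := by
        apply bits_off hmid1.cur.sd.bits hsame
        intro w hw
        have e1 := List.mem_singleton.mp hw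
        subst e1
        simp only []
        omega
      have hmid2 : Mid11 u₀ g i A2 A3 Ai A s_114be6r :=
        hmid1.call hsame hws hb2 hun (w_rsp.trans c_rsp1.symm) ((w_kept.get .r14 rfl).trans c_r14v.symm) w_eq w_inv
      refine ReachVia.done ⟨hmid2, w_rip, ?_⟩
      rw [w_kept.get .r15 rfl]
      exact c_r15

/-- **Leg B3, 0x114beb → 0x114bfc** (`cut153` → the end of C line 3879): `movd ebx, xmm0`, the check of `c->delta_value`, the store. -/
theorem legB3 {Lay : Layout} {μ : Microarch} {u₀ : State} (henv : Env0 Lay μ u₀)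
    (hst4 : Asan.SmallCheck Lay μ Vorbis.WayInv (Vorbis.CodeOK u₀) [.rax, .rcx, .rdx] 4 Vorbis.L.__asan_store4_noabort.entry)
    (g : Ghost) (i : Nat) (A2 A3 Ai : Arena) (A : Arena × List Obj) (v : State)
    (hat : AtPt u₀ g i A2 A3 Ai A Vorbis.L.start_decoder.cut153 v) :
    ReachVia Lay μ WayInv v (fun w => AtPt u₀ g i A2 A3 Ai A 0x114bfc w) := by
  obtain ⟨hLay, hμ, hcode⟩ := henv
  obtain ⟨hmid, hrip, c_r15⟩ := hat
  have he := hmid.fr.entry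
  v_entry he
  have w_rip := hrip
  have c_rsp := rsp_form hmid.fr
  have c_r14 := hmid.cur.r14
  have w_eq : Mem.EqOn Vorbis.L.textLo Vorbis.L.textHi u₀.mem v.mem := hmid.fr.code
  have hdf : v.flags .df = false := (show abiInv _ from hmid.fr.inv).1
  have hmx : v.mxcsr &&& 0x1F80 = 0x1F80 := (show abiInv _ from hmid.fr.inv).2
  have hsse := Vorbis.sseOK_of_abiInv hmid.fr.inv
  simp only [depth] at he_room he_stack
  obtain ⟨hc1, hc2, hc3⟩ := cb_where hmid
  obtain ⟨c, hc⟩ : ∃ c, g.cb v.mem i = c := ⟨_, rfl⟩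
  rw [hc] at c_r14 hc1 hc2 hc3
  u_walk hcode [hμ.vendor] until [0x114bfc] span [Vorbis.L.textLo, Vorbis.L.textHi] side (v_side)
  · -- the check of `c->delta_value`
    have hun : ShadowUntouched v.mem s_114bf3.mem := by v_untouched
    refine check_field hmid hun 20 4 (by omega) (by omega) ?_
    rw [hc]
    simp only [vfield]
    exact toNat_addr _ (by omega)
  · have e : (addr c + 20).toNat = c + 20 := by
      simp only [vfield]
      exact toNat_addr _ (by omega)
    rw [e]
    omega
  · -- `Mid11` after the store
    have hp := hmid.push (L.start_decoder.cut153 + 13).toNat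
    obtain ⟨hp1, hp2, hp3⟩ := cb_where hp
    dsimp only at hp1 hp2 hp3
    have ec : g.cb (v.mem.writeLE (g.e.reg Reg.rsp - 1488) 8 (L.start_decoder.cut153 + 13).toNat) i = c := by
      have h1 := hp.cur.r14
      have h2 : addr (g.cb (v.mem.writeLE (g.e.reg Reg.rsp - 1488) 8 (L.start_decoder.cut153 + 13).toNat) i) = addr c :=
        h1.symm.trans c_r14
      exact addr_inj _ _ (by omega) (by omega) h2
    simp only [vfield] at w_mem
    have hm : Mid11 u₀ g i A2 A3 Ai A s_114bf8 := by
      refine hp.store_field (b := c + 20) (k := 4) w_mem ?_ (w_rsp.trans c_rsp.symm) (w_kept.get .r14 rfl) w_eq ?_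
      · left
        rw [ec]
        omega
      · refine ⟨?_, ?_⟩
        · rw [w_flags]
          exact w_df_114bf3
        · rw [w_mxcsr]
          exact hmx
    refine ReachVia.done ⟨hm, w_rip, ?_⟩
    rw [w_kept.get .r15 rfl]
    exact c_r15

/-- **THE PROVED PREFIX OF SEGMENT C11, 0x114bad → 0x114bfc** (C lines 3878 – 3879: `minimum_value`, `delta_value`; four calls, two
check sites, two field stores): legs A, B1, B2, B3 chained by `ReachVia.trans`. -/
theorem reach_bfc {Lay : Layout} {μ : Microarch} {u₀ : State} (henv : Env0 Lay μ u₀)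
    (h_get_bits : ∀ (others : List Obj) (frames : List (Nat × FrameLayout)) (Blk : Block → Prop) (len : Nat),
      Calls Lay μ Vorbis.WayInv (Vorbis.conv u₀) Vorbis.L.get_bits.entry (Vorbis.Spec.get_bits.spec others frames Blk len))
    (h_f32 : ∀ (others : List Obj) (frames : List (Nat × FrameLayout)),
      Calls Lay μ Vorbis.WayInv (Vorbis.conv u₀) Vorbis.L.float32_unpack.entry (Vorbis.Spec.float32_unpack.spec others frames))
    (hst4 : Asan.SmallCheck Lay μ Vorbis.WayInv (Vorbis.CodeOK u₀) [.rax, .rcx, .rdx] 4 Vorbis.L.__asan_store4_noabort.entry)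
    (g : Ghost) (i : Nat) (A2 A3 Ai : Arena) (A : Arena × List Obj) (v : State) (h : InC11 u₀ g i A2 A3 Ai A v) :
    ReachVia Lay μ WayInv v (fun w => AtPt u₀ g i A2 A3 Ai A 0x114bfc w) := by
  apply ReachVia.trans (legA henv h_get_bits h_f32 g i A2 A3 Ai A v h)
  intro v1 h1
  apply ReachVia.trans (legB1 henv hst4 g i A2 A3 Ai A v1 h1)
  intro v2 h2
  apply ReachVia.trans (legB2 henv h_get_bits h_f32 g i A2 A3 Ai A v2 h2)
  intro v3 h3
  exact legB3 henv hst4 g i A2 A3 Ai A v3 h3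

/-- **Leg C1, 0x114bfc → 0x114c09** (`cut154`; C line 3880 up to the return of `get_bits(f, 4)`): the result is below 16. -/
theorem legC1 {Lay : Layout} {μ : Microarch} {u₀ : State} (henv : Env0 Lay μ u₀)
    (h_get_bits : ∀ (others : List Obj) (frames : List (Nat × FrameLayout)) (Blk : Block → Prop) (len : Nat),
      Calls Lay μ Vorbis.WayInv (Vorbis.conv u₀) Vorbis.L.get_bits.entry (Vorbis.Spec.get_bits.spec others frames Blk len))
    (g : Ghost) (i : Nat) (A2 A3 Ai : Arena) (A : Arena × List Obj) (v : State)
    (hat : AtPt u₀ g i A2 A3 Ai A 0x114bfc v) :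
    ReachVia Lay μ WayInv v
      (fun w => AtPt u₀ g i A2 A3 Ai A Vorbis.L.start_decoder.cut154 w ∧ (w.reg .rax).toNat < 16) := by
  obtain ⟨hLay, hμ, hcode⟩ := henv
  obtain ⟨hmid, hrip, c_r15⟩ := hat
  have he := hmid.fr.entry
  v_entry he
  have w_rip := hrip
  have c_rsp := rsp_form hmid.fr
  have w_eq : Mem.EqOn Vorbis.L.textLo Vorbis.L.textHi u₀.mem v.mem := hmid.fr.code
  have hdf : v.flags .df = false := (show abiInv _ from hmid.fr.inv).1
  have hmx : v.mxcsr &&& 0x1F80 = 0x1F80 := (show abiInv _ from hmid.fr.inv).2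
  have hsse := Vorbis.sseOK_of_abiInv hmid.fr.inv
  have hgb := h_get_bits A.2 g.frames' (g.Blk A) g.len
  simp only [depth] at he_room he_stack
  have hR : g.R = (g.e.reg .rsp).toNat - 1480 := rfl
  obtain ⟨hw1, hw2, hw3⟩ := obj_where hmid.fr hmid.cur.hand
  unfold Ghost.RA at hw3
  have hfdef : g.f = (g.e.reg .rdi).toNat := rfl
  u_walk hcode [hμ.vendor] until [Vorbis.L.start_decoder.cut154] span [Vorbis.L.textLo, Vorbis.L.textHi] side (v_side)
  · v_inv
  · -- pre of get_bits(f, 4)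
    obtain ⟨hsh, hb, hun⟩ := call_pre hmid w_mem w_rsp
    have hrdi : (s_114c04.reg .rdi).toNat = g.f := by
      rw [w_rdi]
      exact toNat_addr g.f (by omega)
    refine ⟨⟨hsh, ?_, ?_⟩, ?_⟩
    · rw [hrdi]
      exact readerEnv hmid.cur.hand hmid.cur.sd.env.live
    · rw [hrdi]
      exact hb
    · rw [bitsArg_def, w_rsi]
      decide
  · v_after_call w_rsp_114c04 w_mem_114c04
    have c_rdi : s_114c04.reg .rdi = g.e.reg .rdi := by
      rw [w_rdi_114c04]
      exact addr_toNat _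
    simp only [c_rdi] at w_same
    obtain ⟨_, _, hun0⟩ := call_pre hmid w_mem_114c04 w_rsp_114c04
    have hun : ShadowUntouched v.mem s_114c04r.mem := Mem.EqOn.trans hun0 w_post.untouched
    have hsame : Mem.SameExcept
        [⟨(g.e.reg .rsp).toNat - 1840, (g.e.reg .rsp).toNat - 1480⟩,
         ⟨(g.e.reg .rdi).toNat + 48, (g.e.reg .rdi).toNat + 56⟩, ⟨(g.e.reg .rdi).toNat + 84, (g.e.reg .rdi).toNat + 96⟩,
         ⟨(g.e.reg .rdi).toNat + 136, (g.e.reg .rdi).toNat + 144⟩, ⟨(g.e.reg .rdi).toNat + 1484, (g.e.reg .rdi).toNat + 1749⟩,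
         ⟨(g.e.reg .rdi).toNat + 1752, (g.e.reg .rdi).toNat + 1784⟩] v.mem s_114c04r.mem := by
      u_same
    have hb1 : Bits (g.Blk A) g.len s_114c04r.mem g.f := by
      have hb := w_post.bits.bits
      rw [c_rdi] at hb
      exact hb
    have hmid1 : Mid11 u₀ g i A2 A3 Ai A s_114c04r := by
      refine hmid.call hsame ?_ hb1 hun (w_rsp.trans c_rsp.symm) (w_kept.get .r14 rfl) w_eq w_inv
      intro w hw
      unfold OffArena Ghost.RA
      simp only [List.mem_cons, List.mem_nil_iff, or_false] at hw
      rcases hw with rfl | rfl | rfl | rfl | rfl | rfl <;> simp only [] <;> omega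
    have hres := w_post.bits.result
    have harg : bitsArg s_114c04 = 4 := by
      rw [bitsArg_def, w_rsi_114c04]
      decide
    rw [harg] at hres
    refine ReachVia.done ⟨⟨hmid1, w_rip, ?_⟩, ?_⟩
    · rw [w_kept.get .r15 rfl]
      exact c_r15
    · have := hres.2 (by omega)
      omega

/-- The byte `lea ebx, [rax+1] ; mov [..], bl` stores when `rax < 16`. -/
theorem low_byte_succ (r : UInt64) (h : r.toNat < 16) :
    (BitVec.setWidth 8 (BitVec.setWidth 32 (r + 1).toBitVec)).toNat = r.toNat + 1 := by
  have e : (r + 1).toNat = r.toNat + 1 := by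
    rw [UInt64.toNat_add]
    have : (1 : UInt64).toNat = 1 := rfl
    omega
  simp only [BitVec.toNat_setWidth, UInt64.toNat_toBitVec, e]
  omega

/-- **Leg C2, 0x114c09 → 0x114c19** (`cut154` → the end of C line 3880): `lea ebx, [rax+1]`, the check of `c->value_bits`, the store; the stored byte is in `[1, 16]`. -/
theorem legC2 {Lay : Layout} {μ : Microarch} {u₀ : State} (henv : Env0 Lay μ u₀)
    (hst1 : Asan.SmallCheck Lay μ Vorbis.WayInv (Vorbis.CodeOK u₀) [.rax, .rdx] 1 Vorbis.L.__asan_store1_noabort.entry)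
    (g : Ghost) (i : Nat) (A2 A3 Ai : Arena) (A : Arena × List Obj) (v : State)
    (hat : AtPt u₀ g i A2 A3 Ai A Vorbis.L.start_decoder.cut154 v) (hrax : (v.reg .rax).toNat < 16) :
    ReachVia Lay μ WayInv v (fun w => AtPt u₀ g i A2 A3 Ai A 0x114c19 w ∧
      1 ≤ Codebook.value_bits w.mem (g.cb w.mem i) ∧ Codebook.value_bits w.mem (g.cb w.mem i) ≤ 16) := by
  obtain ⟨hLay, hμ, hcode⟩ := henv
  obtain ⟨hmid, hrip, c_r15⟩ := hat
  have he := hmid.fr.entry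
  v_entry he
  have w_rip := hrip
  have c_rsp := rsp_form hmid.fr
  have c_r14 := hmid.cur.r14
  have w_eq : Mem.EqOn Vorbis.L.textLo Vorbis.L.textHi u₀.mem v.mem := hmid.fr.code
  have hdf : v.flags .df = false := (show abiInv _ from hmid.fr.inv).1
  have hmx : v.mxcsr &&& 0x1F80 = 0x1F80 := (show abiInv _ from hmid.fr.inv).2
  have hsse := Vorbis.sseOK_of_abiInv hmid.fr.inv
  simp only [depth] at he_room he_stack
  obtain ⟨hc1, hc2, hc3⟩ := cb_where hmid
  obtain ⟨c, hc⟩ : ∃ c, g.cb v.mem i = c := ⟨_, rfl⟩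
  rw [hc] at c_r14 hc1 hc2 hc3
  u_walk hcode [hμ.vendor] until [0x114c19] span [Vorbis.L.textLo, Vorbis.L.textHi] side (v_side)
  · -- the check of `c->value_bits`
    have hun : ShadowUntouched v.mem s_114c10.mem := by v_untouched
    refine check_field hmid hun 24 1 (by omega) (by omega) ?_
    rw [hc]
    simp only [vfield]
    exact toNat_addr _ (by omega)
  · have e : (addr c + 24).toNat = c + 24 := by
      simp only [vfield]
      exact toNat_addr _ (by omega)
    rw [e]
    omega
  · -- `Mid11` after the store
    have hp := hmid.push (L.start_decoder.cut154 + 12).toNat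
    obtain ⟨hp1, hp2, hp3⟩ := cb_where hp
    dsimp only at hp1 hp2 hp3
    have ec : g.cb (v.mem.writeLE (g.e.reg Reg.rsp - 1488) 8 (L.start_decoder.cut154 + 12).toNat) i = c := by
      have h1 := hp.cur.r14
      have h2 : addr (g.cb (v.mem.writeLE (g.e.reg Reg.rsp - 1488) 8 (L.start_decoder.cut154 + 12).toNat) i) = addr c :=
        h1.symm.trans c_r14
      exact addr_inj _ _ (by omega) (by omega) h2
    simp only [vfield] at w_mem
    rw [low_byte_succ _ hrax] at w_mem
    have hm : Mid11 u₀ g i A2 A3 Ai A s_114c15 := by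
      refine hp.store_field (b := c + 24) (k := 1) w_mem ?_ (w_rsp.trans c_rsp.symm) (w_kept.get .r14 rfl) w_eq ?_
      · left
        rw [ec]
        omega
      · refine ⟨?_, ?_⟩
        · rw [w_flags]
          exact w_df_114c10
        · rw [w_mxcsr]
          exact hmx
    obtain ⟨hq1, hq2, hq3⟩ := cb_where hm
    have ec' : g.cb s_114c15.mem i = c := by
      have h1 := hm.cur.r14
      have h2 : addr (g.cb s_114c15.mem i) = addr c := h1.symm.trans ((w_kept.get .r14 rfl).trans c_r14)
      exact addr_inj _ _ (by omega) (by omega) h2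
    have evb : Codebook.value_bits s_114c15.mem c = (v.reg .rax).toNat + 1 := by
      simp only [vacc, voff]
      unfold Mem.u8
      rw [w_mem, Mem.readLE_writeLE_same _ _ 1 _ (by omega)]
      omega
    refine ReachVia.done ⟨⟨hm, w_rip, ?_⟩, ?_⟩
    · rw [w_kept.get .r15 rfl]
      exact c_r15
    · rw [ec', evb]
      omega

/-- **THE PROVED PREFIX OF SEGMENT C11, 0x114bad → 0x114c19** (C lines 3878 – 3880: `minimum_value`, `delta_value`, `value_bits`;
five calls, three check sites, three field stores): `reach_bfc`, legs C1, C2. -/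
theorem reach_c19 {Lay : Layout} {μ : Microarch} {u₀ : State} (henv : Env0 Lay μ u₀)
    (h_get_bits : ∀ (others : List Obj) (frames : List (Nat × FrameLayout)) (Blk : Block → Prop) (len : Nat),
      Calls Lay μ Vorbis.WayInv (Vorbis.conv u₀) Vorbis.L.get_bits.entry (Vorbis.Spec.get_bits.spec others frames Blk len))
    (h_f32 : ∀ (others : List Obj) (frames : List (Nat × FrameLayout)),
      Calls Lay μ Vorbis.WayInv (Vorbis.conv u₀) Vorbis.L.float32_unpack.entry (Vorbis.Spec.float32_unpack.spec others frames))
    (hst4 : Asan.SmallCheck Lay μ Vorbis.WayInv (Vorbis.CodeOK u₀) [.rax, .rcx, .rdx] 4 Vorbis.L.__asan_store4_noabort.entry)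
    (hst1 : Asan.SmallCheck Lay μ Vorbis.WayInv (Vorbis.CodeOK u₀) [.rax, .rdx] 1 Vorbis.L.__asan_store1_noabort.entry)
    (g : Ghost) (i : Nat) (A2 A3 Ai : Arena) (A : Arena × List Obj) (v : State) (h : InC11 u₀ g i A2 A3 Ai A v) :
    ReachVia Lay μ WayInv v (fun w => AtPt u₀ g i A2 A3 Ai A 0x114c19 w ∧
      1 ≤ Codebook.value_bits w.mem (g.cb w.mem i) ∧ Codebook.value_bits w.mem (g.cb w.mem i) ≤ 16) := by
  apply ReachVia.trans (reach_bfc henv h_get_bits h_f32 hst4 g i A2 A3 Ai A v h)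
  intro v1 h1
  apply ReachVia.trans (legC1 henv h_get_bits g i A2 A3 Ai A v1 h1)
  intro v2 h2
  exact legC2 henv hst1 g i A2 A3 Ai A v2 h2.1 h2.2

/-- **The struct `cb(i)` over a call** (the hypotheses of `Mid11.call`): every field reads the same and the struct is where it was —
how `value_bits`, `lookup_values` (facts the segment establishes itself) are carried over the later calls. -/
theorem call_fields {u₀ : State} {g : Ghost} {i : Nat} {A2 A3 Ai : Arena} {A : Arena × List Obj} {v : State} {mem' : Mem}
    (h : Mid11 u₀ g i A2 A3 Ai A v) {ws : List Span} (hs : Mem.SameExcept ws v.mem mem') (hws : ∀ w, w ∈ ws → OffArena g w) :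
    g.cb mem' i = g.cb v.mem i ∧ Codebook.SameFields v.mem mem' (g.cb v.mem i) := by
  obtain ⟨hfr, hcur, hbook, hno⟩ := h
  obtain ⟨hw1, hw2, hw3⟩ := obj_where hfr hcur.hand
  obtain ⟨hra1, hra2, hra3⟩ := hfr.ra
  obtain ⟨hr1, hr2⟩ := hfr.r_eq
  simp only [depth, steady] at hra2 hr1
  have ha := hcur.sd.arena
  have hout := hcur.objOut
  simp only [Off.sizeof.stb_vorbis] at hout
  have ecbs : stb_vorbis.codebooks mem' g.f = stb_vorbis.codebooks v.mem g.f := by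
    simp only [vacc, voff]
    unfold Mem.u64
    apply hs.readLE
    · rw [toNat_addr _ (by omega)]
      omega
    · intro w hw
      rw [toNat_addr _ (by omega)]
      have := hws w hw
      unfold OffArena at this
      omega
  have hk : AllKept A.1.Blk v.mem mem' := by
    apply AllKept.of_sameExcept ha.blkOK hs
    intro B hB w hw
    have h1 := ha.blk_off_stack hB
    have h2 := arena_inside ha hB
    have := hws w hw
    unfold OffArena at this
    omega
  have hcb := hcur.ages.cbOK
  have hcbA : A.1.Blk (codebooksBlock v.mem g.f) := hcb.F2.mono hcur.ages.exti
  refine ⟨?_, Codebook.SameFields.of_kept (hcb.cb_kept (hk _ hcbA) i hcur.lt)⟩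
  unfold Ghost.cb
  simp only [stb_vorbis.codebooks_at]
  rw [ecbs]

/-- `value_bits` over a store that misses the byte `c + 18H`. -/
theorem store_keeps_vb (mem : Mem) (c b k x : Nat) (hc : c + 2120 ≤ 2 ^ 64) (hb : b + k ≤ 2 ^ 64) (hb' : b < 2 ^ 64)
    (hd : b + k ≤ c + 0x18 ∨ c + 0x19 ≤ b) :
    Codebook.value_bits (mem.writeLE (addr b) k x) c = Codebook.value_bits mem c := by
  simp only [vacc, voff]
  apply Mem.u8_writeLE
  · rw [toNat_addr b hb']
    exact hb
  · omega
  · rw [toNat_addr b hb']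
    omega

/-- **Leg D1, 0x114c19 → 0x114c26** (`cut155`; C line 3881 up to the return of `get_bits(f, 1)`); `value_bits ∈ [1, 16]` is carried. -/
theorem legD1 {Lay : Layout} {μ : Microarch} {u₀ : State} (henv : Env0 Lay μ u₀)
    (h_get_bits : ∀ (others : List Obj) (frames : List (Nat × FrameLayout)) (Blk : Block → Prop) (len : Nat),
      Calls Lay μ Vorbis.WayInv (Vorbis.conv u₀) Vorbis.L.get_bits.entry (Vorbis.Spec.get_bits.spec others frames Blk len))
    (g : Ghost) (i : Nat) (A2 A3 Ai : Arena) (A : Arena × List Obj) (v : State)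
    (hat : AtPt u₀ g i A2 A3 Ai A 0x114c19 v)
    (hvb : 1 ≤ Codebook.value_bits v.mem (g.cb v.mem i) ∧ Codebook.value_bits v.mem (g.cb v.mem i) ≤ 16) :
    ReachVia Lay μ WayInv v
      (fun w => AtPt u₀ g i A2 A3 Ai A Vorbis.L.start_decoder.cut155 w ∧
        (1 ≤ Codebook.value_bits w.mem (g.cb w.mem i) ∧ Codebook.value_bits w.mem (g.cb w.mem i) ≤ 16)) := by
  obtain ⟨hLay, hμ, hcode⟩ := henv
  obtain ⟨hmid, hrip, c_r15⟩ := hat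
  have he := hmid.fr.entry
  v_entry he
  have w_rip := hrip
  have c_rsp := rsp_form hmid.fr
  have w_eq : Mem.EqOn Vorbis.L.textLo Vorbis.L.textHi u₀.mem v.mem := hmid.fr.code
  have hdf : v.flags .df = false := (show abiInv _ from hmid.fr.inv).1
  have hmx : v.mxcsr &&& 0x1F80 = 0x1F80 := (show abiInv _ from hmid.fr.inv).2
  have hsse := Vorbis.sseOK_of_abiInv hmid.fr.inv
  have hgb := h_get_bits A.2 g.frames' (g.Blk A) g.len
  simp only [depth] at he_room he_stack
  have hR : g.R = (g.e.reg .rsp).toNat - 1480 := rfl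
  obtain ⟨hw1, hw2, hw3⟩ := obj_where hmid.fr hmid.cur.hand
  unfold Ghost.RA at hw3
  have hfdef : g.f = (g.e.reg .rdi).toNat := rfl
  u_walk hcode [hμ.vendor] until [Vorbis.L.start_decoder.cut155] span [Vorbis.L.textLo, Vorbis.L.textHi] side (v_side)
  · v_inv
  · -- pre of get_bits(f, 4)
    obtain ⟨hsh, hb, hun⟩ := call_pre hmid w_mem w_rsp
    have hrdi : (s_114c21.reg .rdi).toNat = g.f := by
      rw [w_rdi]
      exact toNat_addr g.f (by omega)
    refine ⟨⟨hsh, ?_, ?_⟩, ?_⟩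
    · rw [hrdi]
      exact readerEnv hmid.cur.hand hmid.cur.sd.env.live
    · rw [hrdi]
      exact hb
    · rw [bitsArg_def, w_rsi]
      decide
  · v_after_call w_rsp_114c21 w_mem_114c21
    have c_rdi : s_114c21.reg .rdi = g.e.reg .rdi := by
      rw [w_rdi_114c21]
      exact addr_toNat _
    simp only [c_rdi] at w_same
    obtain ⟨_, _, hun0⟩ := call_pre hmid w_mem_114c21 w_rsp_114c21
    have hun : ShadowUntouched v.mem s_114c21r.mem := Mem.EqOn.trans hun0 w_post.untouched
    have hsame : Mem.SameExcept
        [⟨(g.e.reg .rsp).toNat - 1840, (g.e.reg .rsp).toNat - 1480⟩,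
         ⟨(g.e.reg .rdi).toNat + 48, (g.e.reg .rdi).toNat + 56⟩, ⟨(g.e.reg .rdi).toNat + 84, (g.e.reg .rdi).toNat + 96⟩,
         ⟨(g.e.reg .rdi).toNat + 136, (g.e.reg .rdi).toNat + 144⟩, ⟨(g.e.reg .rdi).toNat + 1484, (g.e.reg .rdi).toNat + 1749⟩,
         ⟨(g.e.reg .rdi).toNat + 1752, (g.e.reg .rdi).toNat + 1784⟩] v.mem s_114c21r.mem := by
      u_same
    have hb1 : Bits (g.Blk A) g.len s_114c21r.mem g.f := by
      have hb := w_post.bits.bits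
      rw [c_rdi] at hb
      exact hb
    have hmid1 : Mid11 u₀ g i A2 A3 Ai A s_114c21r := by
      refine hmid.call hsame ?_ hb1 hun (w_rsp.trans c_rsp.symm) (w_kept.get .r14 rfl) w_eq w_inv
      intro w hw
      unfold OffArena Ghost.RA
      simp only [List.mem_cons, List.mem_nil_iff, or_false] at hw
      rcases hw with rfl | rfl | rfl | rfl | rfl | rfl <;> simp only [] <;> omega
    have hws : ∀ w, w ∈ [(⟨(g.e.reg .rsp).toNat - 1840, (g.e.reg .rsp).toNat - 1480⟩ : Span),
        ⟨(g.e.reg .rdi).toNat + 48, (g.e.reg .rdi).toNat + 56⟩, ⟨(g.e.reg .rdi).toNat + 84, (g.e.reg .rdi).toNat + 96⟩,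
        ⟨(g.e.reg .rdi).toNat + 136, (g.e.reg .rdi).toNat + 144⟩, ⟨(g.e.reg .rdi).toNat + 1484, (g.e.reg .rdi).toNat + 1749⟩,
        ⟨(g.e.reg .rdi).toNat + 1752, (g.e.reg .rdi).toNat + 1784⟩] → OffArena g w := by
      intro w hw
      unfold OffArena Ghost.RA
      simp only [List.mem_cons, List.mem_nil_iff, or_false] at hw
      rcases hw with rfl | rfl | rfl | rfl | rfl | rfl <;> simp only [] <;> omega
    obtain ⟨ecb, esf⟩ := call_fields hmid hsame hws
    refine ReachVia.done ⟨⟨hmid1, w_rip, ?_⟩, ?_⟩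
    · rw [w_kept.get .r15 rfl]
      exact c_r15
    · rw [ecb, esf.value_bits]
      exact hvb

/-- **Leg D2, 0x114c26 → 0x114c35** (`cut155` → the end of C line 3881): the check of `c->sequence_p`, the store (any byte); `value_bits ∈ [1, 16]` is carried. -/
theorem legD2 {Lay : Layout} {μ : Microarch} {u₀ : State} (henv : Env0 Lay μ u₀)
    (hst1 : Asan.SmallCheck Lay μ Vorbis.WayInv (Vorbis.CodeOK u₀) [.rax, .rdx] 1 Vorbis.L.__asan_store1_noabort.entry)
    (g : Ghost) (i : Nat) (A2 A3 Ai : Arena) (A : Arena × List Obj) (v : State)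
    (hat : AtPt u₀ g i A2 A3 Ai A Vorbis.L.start_decoder.cut155 v) 
    (hvb : 1 ≤ Codebook.value_bits v.mem (g.cb v.mem i) ∧ Codebook.value_bits v.mem (g.cb v.mem i) ≤ 16) :
    ReachVia Lay μ WayInv v (fun w => AtPt u₀ g i A2 A3 Ai A 0x114c35 w ∧
      1 ≤ Codebook.value_bits w.mem (g.cb w.mem i) ∧ Codebook.value_bits w.mem (g.cb w.mem i) ≤ 16) := by
  obtain ⟨hLay, hμ, hcode⟩ := henv
  obtain ⟨hmid, hrip, c_r15⟩ := hat
  have he := hmid.fr.entry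
  v_entry he
  have w_rip := hrip
  have c_rsp := rsp_form hmid.fr
  have c_r14 := hmid.cur.r14
  have w_eq : Mem.EqOn Vorbis.L.textLo Vorbis.L.textHi u₀.mem v.mem := hmid.fr.code
  have hdf : v.flags .df = false := (show abiInv _ from hmid.fr.inv).1
  have hmx : v.mxcsr &&& 0x1F80 = 0x1F80 := (show abiInv _ from hmid.fr.inv).2
  have hsse := Vorbis.sseOK_of_abiInv hmid.fr.inv
  simp only [depth] at he_room he_stack
  obtain ⟨hc1, hc2, hc3⟩ := cb_where hmid
  obtain ⟨c, hc⟩ : ∃ c, g.cb v.mem i = c := ⟨_, rfl⟩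
  rw [hc] at c_r14 hc1 hc2 hc3
  u_walk hcode [hμ.vendor] until [0x114c35] span [Vorbis.L.textLo, Vorbis.L.textHi] side (v_side)
  · -- the check of `c->value_bits`
    have hun : ShadowUntouched v.mem s_114c2c.mem := by v_untouched
    refine check_field hmid hun 26 1 (by omega) (by omega) ?_
    rw [hc]
    simp only [vfield]
    exact toNat_addr _ (by omega)
  · have e : (addr c + 26).toNat = c + 26 := by
      simp only [vfield]
      exact toNat_addr _ (by omega)
    rw [e]
    omega
  · -- `Mid` after the store
    have hp := hmid.push (L.start_decoder.cut155 + 11).toNat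
    obtain ⟨hp1, hp2, hp3⟩ := cb_where hp
    dsimp only at hp1 hp2 hp3
    have ec : g.cb (v.mem.writeLE (g.e.reg Reg.rsp - 1488) 8 (L.start_decoder.cut155 + 11).toNat) i = c := by
      have h1 := hp.cur.r14
      have h2 : addr (g.cb (v.mem.writeLE (g.e.reg Reg.rsp - 1488) 8 (L.start_decoder.cut155 + 11).toNat) i) = addr c :=
        h1.symm.trans c_r14
      exact addr_inj _ _ (by omega) (by omega) h2
    simp only [vfield] at w_mem
    have hm : Mid11 u₀ g i A2 A3 Ai A s_114c31 := by
      refine hp.store_field (b := c + 26) (k := 1) w_mem ?_ (w_rsp.trans c_rsp.symm) (w_kept.get .r14 rfl) w_eq ?_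
      · right
        left
        rw [ec]
        omega
      · refine ⟨?_, ?_⟩
        · rw [w_flags]
          exact w_df_114c2c
        · rw [w_mxcsr]
          exact hmx
    obtain ⟨hq1, hq2, hq3⟩ := cb_where hm
    have ec' : g.cb s_114c31.mem i = c := by
      have h1 := hm.cur.r14
      have h2 : addr (g.cb s_114c31.mem i) = addr c := h1.symm.trans ((w_kept.get .r14 rfl).trans c_r14)
      exact addr_inj _ _ (by omega) (by omega) h2
    -- `value_bits` through the pushed return address and the store
    have hsp : Mem.SameExcept [⟨g.RA - 1488, g.RA - 1480⟩] v.mem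
        (v.mem.writeLE (g.e.reg .rsp - 1488) 8 (L.start_decoder.cut155 + 11).toNat) := by
      apply Mem.SameExcept.writeLE
      · u_omega
      · refine ⟨_, List.mem_cons_self, ?_, ?_⟩
        · simp only []
          unfold Ghost.RA
          u_omega
        · simp only []
          unfold Ghost.RA
          u_omega
    have hwsp : ∀ w, w ∈ [(⟨g.RA - 1488, g.RA - 1480⟩ : Span)] → OffArena g w := by
      intro w hw
      have e1 := List.mem_singleton.mp hw
      subst e1
      have hR : g.R = (g.e.reg .rsp).toNat - 1480 := rfl
      unfold OffArena Ghost.RA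
      simp only []
      omega
    obtain ⟨_, esf⟩ := call_fields hmid hsp hwsp
    have evb : Codebook.value_bits s_114c31.mem c = Codebook.value_bits v.mem c := by
      rw [w_mem, store_keeps_vb _ c (c + 26) 1 _ (by omega) (by omega) (by omega) (by omega)]
      rw [← hc]
      exact esf.value_bits
    refine ReachVia.done ⟨⟨hm, w_rip, ?_⟩, ?_⟩
    · rw [w_kept.get .r15 rfl]
      exact c_r15
    · rw [ec', evb, ← hc]
      exact hvb

/-- **THE PROVED PREFIX OF SEGMENT C11, 0x114bad → 0x114c35** (C lines 3878 – 3881: `minimum_value`, `delta_value`, `value_bits`,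
`sequence_p`; six calls, four check sites, four field stores): `reach_c19`, legs D1, D2. -/
theorem reach_c35 {Lay : Layout} {μ : Microarch} {u₀ : State} (henv : Env0 Lay μ u₀)
    (h_get_bits : ∀ (others : List Obj) (frames : List (Nat × FrameLayout)) (Blk : Block → Prop) (len : Nat),
      Calls Lay μ Vorbis.WayInv (Vorbis.conv u₀) Vorbis.L.get_bits.entry (Vorbis.Spec.get_bits.spec others frames Blk len))
    (h_f32 : ∀ (others : List Obj) (frames : List (Nat × FrameLayout)),
      Calls Lay μ Vorbis.WayInv (Vorbis.conv u₀) Vorbis.L.float32_unpack.entry (Vorbis.Spec.float32_unpack.spec others frames))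
    (hst4 : Asan.SmallCheck Lay μ Vorbis.WayInv (Vorbis.CodeOK u₀) [.rax, .rcx, .rdx] 4 Vorbis.L.__asan_store4_noabort.entry)
    (hst1 : Asan.SmallCheck Lay μ Vorbis.WayInv (Vorbis.CodeOK u₀) [.rax, .rdx] 1 Vorbis.L.__asan_store1_noabort.entry)
    (g : Ghost) (i : Nat) (A2 A3 Ai : Arena) (A : Arena × List Obj) (v : State) (h : InC11 u₀ g i A2 A3 Ai A v) :
    ReachVia Lay μ WayInv v (fun w => AtPt u₀ g i A2 A3 Ai A 0x114c35 w ∧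
      1 ≤ Codebook.value_bits w.mem (g.cb w.mem i) ∧ Codebook.value_bits w.mem (g.cb w.mem i) ≤ 16) := by
  apply ReachVia.trans (reach_c19 henv h_get_bits h_f32 hst4 hst1 g i A2 A3 Ai A v h)
  intro v1 h1
  apply ReachVia.trans (legD1 henv h_get_bits g i A2 A3 Ai A v1 h1.1 h1.2)
  intro v2 h2
  exact legD2 henv hst1 g i A2 A3 Ai A v2 h2.1 h2.2

/-- The windows of `*f` that `SDw 3` reads besides `Bits` and the arena's four fields: `cfgWins` without `[96, 136)`'s tail
`temp_offset` (`[132, 136)`, which `setup_temp_malloc` stores). -/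
def cfgWinsT : Wins := [(0, 48), (56, 84), (96, 132), (144, 1484), (1749, 1752), (1784, 1808)]

/-- A span `setup_temp_malloc` may write: the stack below `R`, `temp_offset`, the shadow of the arena. -/
def TempSpan (g : Ghost) (A : Arena) (w : Span) : Prop :=
  (g.RA - 1888 ≤ w.lo ∧ w.hi ≤ g.R) ∨ (g.f + 132 ≤ w.lo ∧ w.hi ≤ g.f + 136) ∨
    (0xC00000 + A.B / 8 ≤ w.lo ∧ w.hi ≤ 0xC00000 + (A.B + A.L + 7) / 8)

/-- **THE ARENA TRANSITION OF `setup_temp_malloc` (success)**: from `Mid11` at `v` (arena `A`, no temp block) to the common part `Frame`,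
CUR(i) and the book under construction at the returned state `s` for the arena `(A.1.pushTemp n, A.1.newTempObj n :: A.2)` — given the
callee's post (`ArenaOK`, `ShadowInv` for the new object list) and its footprint. (`Cur.grow` cannot be used here: it asks for
`Cur … A s`, whose `ArenaOK A.1` is false at the return memory.) -/
theorem temp_transition {u₀ : State} {g : Ghost} {i : Nat} {A2 A3 Ai : Arena} {A : Arena × List Obj} {v s : State}
    (h : Mid11 u₀ g i A2 A3 Ai A v) (n : Nat) {ws : List Span} (hs : Mem.SameExcept ws v.mem s.mem)
    (hws : ∀ w, w ∈ ws → TempSpan g A.1 w)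
    (harena : ArenaOK (A.1.pushTemp n) (A.1.newTempObj n :: A.2) s.mem g.f)
    (hshadow : ShadowInv (A.1.newTempObj n :: A.2) g.frames' g.R s.mem)
    (hrsp : s.reg .rsp = v.reg .rsp) (hr14 : s.reg .r14 = v.reg .r14) (hcode : CodeOK u₀ s.mem) (hinv : abiInv s) :
    Frame u₀ g s.rip (A.1.pushTemp n, A.1.newTempObj n :: A.2) s ∧
      Cur g i A2 A3 Ai (A.1.pushTemp n, A.1.newTempObj n :: A.2) s ∧
      Book11 g i Ai (A.1.pushTemp n, A.1.newTempObj n :: A.2) s.mem ∧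
      g.cb s.mem i = g.cb v.mem i ∧ Codebook.SameFields v.mem s.mem (g.cb v.mem i) := by
  obtain ⟨hfr, hcur, hbook, hno⟩ := h
  obtain ⟨hw1, hw2, hw3⟩ := obj_where hfr hcur.hand
  obtain ⟨hra1, hra2, hra3⟩ := hfr.ra
  obtain ⟨hr1, hr2⟩ := hfr.r_eq
  simp only [depth, steady] at hra2 hr1
  have ha := hcur.sd.arena
  have hout := hcur.objOut
  simp only [Off.sizeof.stb_vorbis] at hout
  have hbnd := ha.bounds
  have hstack : ∀ lo hi, g.R ≤ lo → hi ≤ g.RA + 8 → Mem.EqOn lo hi v.mem s.mem := by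
    intro lo hi h1 h2
    apply hs.eqOn
    intro w hw
    have := hws w hw
    unfold TempSpan at this
    omega
  have he : ObjEq cfgWinsT v.mem g.f s.mem g.f := by
    apply ObjEq.of_sameExcept hs
    · intro w hw
      simp only [cfgWinsT, List.mem_cons, List.mem_nil_iff, or_false] at hw
      rcases hw with rfl | rfl | rfl | rfl | rfl | rfl <;> simp only [] <;> omega
    · intro w hw sp hsp
      have := hws sp hsp
      unfold TempSpan at this
      simp only [cfgWinsT, List.mem_cons, List.mem_nil_iff, or_false] at hw
      rcases hw with rfl | rfl | rfl | rfl | rfl | rfl <;> simp only [] <;> omega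
  have hk : AllKept A.1.Blk v.mem s.mem := by
    apply AllKept.of_sameExcept ha.blkOK hs
    intro B hB w hw
    have h1 := ha.blk_off_stack hB
    have h2 := arena_inside ha hB
    have := hws w hw
    unfold TempSpan at this
    omega
  have ecbs : stb_vorbis.codebooks s.mem g.f = stb_vorbis.codebooks v.mem g.f := by
    simp only [vacc, voff]
    exact he.u64 168 (by decide)
  have ecnt : stb_vorbis.codebook_count s.mem g.f = stb_vorbis.codebook_count v.mem g.f := by
    simp only [vacc, voff]
    exact he.i32 160 (by decide)
  have ecb : g.cb s.mem i = g.cb v.mem i := by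
    unfold Ghost.cb
    simp only [stb_vorbis.codebooks_at]
    rw [ecbs]
  have hext : A.1.Extends (A.1.pushTemp n) := A.1.extends_pushTemp n
  have hsub : ∀ o, o ∈ A.2 → o ∈ A.1.newTempObj n :: A.2 := fun o ho => List.mem_cons_of_mem _ ho
  have hhand : g.Hand (A.1.pushTemp n, A.1.newTempObj n :: A.2) := HandOK.mono hcur.hand hext hsub
  have hblk : g.Blk (A.1.pushTemp n, A.1.newTempObj n :: A.2) = g.Blk A := rfl
  have hlive : ∀ x, g.Live A x → g.Live (A.1.pushTemp n, A.1.newTempObj n :: A.2) x := by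
    intro x hx
    obtain ⟨o, ho, hb⟩ := hx
    refine ⟨o, ?_, hb⟩
    rcases List.mem_append.mp ho with h1 | h2
    · exact List.mem_append_left _ h1
    · exact List.mem_append_right _ (hsub o h2)
  have hb : Bits (g.Blk A) g.len s.mem g.f := by
    apply hcur.sd.bits.frame_fields
    apply Bits.SameFields.of_sameExcept hs
    all_goals
      intro w hw
      have := hws w hw
      unfold TempSpan at this
      omega
  have hsd : SDw g.len 3 (A.1.pushTemp n, A.1.newTempObj n :: A.2) (g.Blk (A.1.pushTemp n, A.1.newTempObj n :: A.2))
      (g.Live (A.1.pushTemp n, A.1.newTempObj n :: A.2)) s.mem g.f g.R := by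
    rw [hblk]
    refine
      { env := ⟨hshadow.shadow.covers, hcur.sd.env.ok, BlkLive.mono hcur.sd.env.live hlive⟩
        frame := hcur.sd.frame.frame (hstack _ _ (by omega) (by omega)) (by omega)
        arena := harena
        setups := fun B hB => up g A B hB
        bits := hb
        first := ?_
        discard0 := ?_
        header := fun hk' => (hcur.sd.header hk').transfer (he.sub (by decide))
        cb0 := fun hk' => ⟨(hcur.sd.cb0 hk').1.transfer (he.sub (by decide)) (fun _ _ hB => hB), ?_⟩
        rest := ?_ }
    · have h1 := hcur.sd.first
      simp only [vacc, voff] at h1 ⊢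
      rw [he.u8 1749 (by decide)]
      exact h1
    · have h1 := hcur.sd.discard0
      simp only [vacc, voff] at h1 ⊢
      rw [he.i32 1784 (by decide)]
      exact h1
    · rw [ecbs]
      exact (hcur.sd.cb0 hk').2
    · have h1 := hcur.sd.rest
      unfold RestZero restFrom at h1 ⊢
      simp only [voff] at h1 ⊢
      have e : (if 3 ≤ 2 then 160 else if 3 ≤ 5 then 176 else if 3 = 6 then 320 else if 3 = 7 then 464 else
          if 3 = 8 then 480 else if 3 = 9 then 868 else if 3 = 10 then 1400 else 1480) = 176 := by decide
      rw [e] at h1 ⊢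
      intro o ho1 ho2
      have hm : ((144, 1484) : Nat × Nat) ∈ cfgWinsT := by decide
      rw [he (144, 1484) hm o (by simp only []; omega) (by simp only []; omega)]
      exact h1 o ho1 ho2
  have hF1 := hcur.ages.F1
  have hlt := hcur.lt
  have hcb := hcur.ages.cbOK
  have hcbA : A.1.Blk (codebooksBlock v.mem g.f) := hcb.F2.mono hcur.ages.exti
  have hkcb := hk _ hcbA
  have hcur' : Cur g i A2 A3 Ai (A.1.pushTemp n, A.1.newTempObj n :: A.2) s := by
    refine
      { sd := hsd
        hand := hhand
        ages := (hcur.ages.frame_old (he.sub (by decide)) (fun B hB => hk B (hB.mono hcur.ages.exti))).grow hext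
        zf := ?_
        lt := ?_
        slot_f := ?_
        slot_i := ?_
        r14 := ?_ }
    · rw [ecbs, ecnt]
      have hw := hkcb.inside
      have hsm := hkcb.same
      simp only [vblock] at hw hsm
      apply hcur.zf.same
      · apply Mem.EqOn.mono hsm
        · simp only [voff]
          omega
        · exact Nat.le_refl _
      · omega
      · exact hw
    · rw [ecnt]
      exact hcur.lt
    · rw [← hcur.slot_f]
      exact (hstack (g.R + 0x18) (g.R + 0x20) (by omega) (by omega)).u64 (g.R + 0x18) (by omega) (by omega) (by omega)
    · rw [← hcur.slot_i]
      exact (hstack (g.R + 0x30) (g.R + 0x34) (by omega) (by omega)).u32 (g.R + 0x30) (by omega) (by omega) (by omega)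
    · rw [hr14, ecb]
      exact hcur.r14
  have hbook0 : Book11 g i Ai A s.mem := Book11.transport hcur hbook ecb hk
  have hbook' : Book11 g i Ai (A.1.pushTemp n, A.1.newTempObj n :: A.2) s.mem :=
    ⟨K15.mono hbook0.k (fun B hB => hB.mono hext), hbook0.type_12, hbook0.prod_le, hbook0.mu0⟩
  have hlog : Log2_4In s.mem := by
    apply log2_carry hfr.sh7 hs
    intro w hw
    have hol := obj_off_log2 hcur.sd.env.ok
    have := hws w hw
    unfold TempSpan at this
    omega
  refine ⟨?_, hcur', hbook', ecb, Codebook.SameFields.of_kept (hcb.cb_kept hkcb i hcur.lt)⟩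
  have e8 := hstack (g.R + 8) (g.R + 16) (by omega) (by omega)
  have esv := hstack (g.R + 0x598) (g.R + 0x5d0) (by omega) (by omega)
  refine
    { entry := hfr.entry
      rip := rfl
      rsp := hrsp.trans hfr.rsp
      shadowIdx := (e8.u64 (g.R + 8) (by omega) (by omega) (by omega)).trans hfr.shadowIdx
      saved_rbx := (esv.u64 (g.R + 0x598) (by omega) (by omega) (by omega)).trans hfr.saved_rbx
      saved_rbp := (esv.u64 (g.R + 0x5a0) (by omega) (by omega) (by omega)).trans hfr.saved_rbp
      saved_r12 := (esv.u64 (g.R + 0x5a8) (by omega) (by omega) (by omega)).trans hfr.saved_r12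
      saved_r13 := (esv.u64 (g.R + 0x5b0) (by omega) (by omega) (by omega)).trans hfr.saved_r13
      saved_r14 := (esv.u64 (g.R + 0x5b8) (by omega) (by omega) (by omega)).trans hfr.saved_r14
      saved_r15 := (esv.u64 (g.R + 0x5c0) (by omega) (by omega) (by omega)).trans hfr.saved_r15
      saved_ra := (esv.u64 (g.R + 0x5c8) (by omega) (by omega) (by omega)).trans hfr.saved_ra
      code := hcode
      inv := hinv
      shadow := hshadow
      offText := ?_
      ext := hfr.ext.trans hext
      callers := hfr.callers
      sh7 := hlog
      same := ?_ }
  · intro o ho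
    rcases List.mem_cons.mp ho with rfl | h2
    · have htx := hcur.hand.arenaText
      show L.textHi ≤ A.1.B + (A.1.T - (r8 n + 32))
      omega
    · exact hfr.offText o h2
  · apply hfr.same.trans
    apply hs.mono
    intro w hw a h1 h2
    have := hws w hw
    unfold TempSpan at this
    have eB := hfr.ext.B
    have eL := hfr.ext.L
    rcases this with h0 | h0 | h0
    · refine ⟨⟨g.RA - depth, g.RA⟩, List.mem_cons_self, ?_, ?_⟩
      · show g.RA - depth ≤ a
        simp only [depth]
        omega
      · show a < g.RA
        omega
    · refine ⟨(objBlock (g.e.reg .rdi).toNat).span, List.mem_cons_of_mem _ List.mem_cons_self, ?_, ?_⟩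
      · show g.f ≤ a
        omega
      · show a < g.f + Off.sizeof.stb_vorbis
        simp only [Off.sizeof.stb_vorbis]
        omega
    · refine ⟨shadowSpan g.A0.1.B (g.A0.1.B + g.A0.1.L), ?_, ?_, ?_⟩
      · unfold footprint writes
        simp only [List.mem_cons, true_or, or_true]
      · show 0xC00000 + g.A0.1.B / 8 ≤ a
        rw [← eB]
        omega
      · show a < 0xC00000 + (g.A0.1.B + g.A0.1.L + 7) / 8
        rw [← eB, ← eL]
        omega

/-- `cur_transport` with the frame slots in two ranges, `[R+8, R+28H)` and `[R+30H, R+34H)`: the spill slot of `mults`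
`[R+28H, R+30H)` between them may change. -/
theorem cur_transport2 {g : Ghost} {i : Nat} {A2 A3 Ai : Arena} {A : Arena × List Obj} {v s : State}
    (h : Cur g i A2 A3 Ai A v) (hr14 : s.reg .r14 = v.reg .r14)
    (hb : Bits (g.Blk A) g.len s.mem g.f) (hsh : ShadowUntouched v.mem s.mem)
    (hst : Mem.EqOn (g.R + 8) (g.R + 0x28) v.mem s.mem) (hst2 : Mem.EqOn (g.R + 0x30) (g.R + 0x34) v.mem s.mem)
    (hR : g.R + 0x38 ≤ 2 ^ 64)
    (he : ObjEq cfgWins v.mem g.f s.mem g.f) (hk : AllKept A.1.Blk v.mem s.mem) : Cur g i A2 A3 Ai A s := by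
  have ecbs : stb_vorbis.codebooks s.mem g.f = stb_vorbis.codebooks v.mem g.f := by
    simp only [vacc, voff]
    exact he.u64 168 (by decide)
  have ecnt : stb_vorbis.codebook_count s.mem g.f = stb_vorbis.codebook_count v.mem g.f := by
    simp only [vacc, voff]
    exact he.i32 160 (by decide)
  have ecb : g.cb s.mem i = g.cb v.mem i := by
    unfold Ghost.cb
    simp only [stb_vorbis.codebooks_at]
    rw [ecbs]
  have hcb := h.ages.cbOK
  have hcbA : A.1.Blk (codebooksBlock v.mem g.f) := hcb.F2.mono h.ages.exti
  have hkcb := hk _ hcbA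
  have hF1 := h.ages.F1
  refine
    { sd := sdw_transport h.sd hb hsh hst (by omega) he
      hand := h.hand
      ages := h.ages.frame_old (he.sub (by decide)) (fun B hB => hk B (hB.mono h.ages.exti))
      zf := ?_
      lt := ?_
      slot_f := ?_
      slot_i := ?_
      r14 := ?_ }
  · rw [ecbs, ecnt]
    have hlt := h.lt
    have hw := hkcb.inside
    have hsm := hkcb.same
    simp only [vblock] at hw hsm
    apply h.zf.same
    · apply Mem.EqOn.mono hsm
      · simp only [voff]
        omega
      · exact Nat.le_refl _
    · omega
    · exact hw
  · rw [ecnt]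
    exact h.lt
  · rw [← h.slot_f]
    exact hst.u64 (g.R + 0x18) (by omega) (by omega) (by omega)
  · rw [← h.slot_i]
    exact hst2.u32 (g.R + 0x30) (by omega) (by omega) (by omega)
  · rw [hr14, ecb]
    exact h.r14

/-- A span the segment may write once the temp block `mults` is there (the loop of line 3892): `OffArena` (the stack below `R`, the
reader windows of `*f`), the spill slot of `mults` `[R+28H, R+30H)`, or a range inside the temp block `⟨q, m⟩`. -/
def LoopSpan (g : Ghost) (q m : Nat) (w : Span) : Prop :=
  OffArena g w ∨ (g.R + 0x28 ≤ w.lo ∧ w.hi ≤ g.R + 0x30) ∨ (q ≤ w.lo ∧ w.hi ≤ q + m)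

/-- **`Frame`, CUR(i) and the book under construction OVER ANY FOOTPRINT OF `LoopSpan`s, for any arena** (temp blocks outstanding,
or none: `q = 0`, `m = 0` — the failed `setup_temp_malloc`, whose NULL result is spilled all the same):
`Mid11.call` without `temps = []`, with the spill of `mults` and the stores into the temp block — the transport of the loop of line
3892 (its `get_bits`, its `mults[j] = q`) and of `mov [rsp+28H], rax`. -/
theorem trip_transport {u₀ : State} {g : Ghost} {i : Nat} {A2 A3 Ai : Arena} {A : Arena × List Obj} {v s : State}
    (hfr : Frame u₀ g v.rip A v) (hcur : Cur g i A2 A3 Ai A v) (hbook : Book11 g i Ai A v.mem)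
    {q m : Nat} (hq : A.1.TBlock q m ∨ (q = 0 ∧ m = 0)) {ws : List Span} (hs : Mem.SameExcept ws v.mem s.mem)
    (hws : ∀ w, w ∈ ws → LoopSpan g q m w)
    (hb : Bits (g.Blk A) g.len s.mem g.f) (hsh : ShadowUntouched v.mem s.mem) (hrsp : s.reg .rsp = v.reg .rsp)
    (hr14 : s.reg .r14 = v.reg .r14) (hcode : CodeOK u₀ s.mem) (hinv : abiInv s) :
    Frame u₀ g s.rip A s ∧ Cur g i A2 A3 Ai A s ∧ Book11 g i Ai A s.mem ∧
      g.cb s.mem i = g.cb v.mem i ∧ Codebook.SameFields v.mem s.mem (g.cb v.mem i) := by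
  obtain ⟨hw1, hw2, hw3⟩ := obj_where hfr hcur.hand
  obtain ⟨hra1, hra2, hra3⟩ := hfr.ra
  obtain ⟨hr1, hr2⟩ := hfr.r_eq
  simp only [depth, steady] at hra2 hr1
  have ha := hcur.sd.arena
  have hout := hcur.objOut
  simp only [Off.sizeof.stb_vorbis] at hout
  have hbnd := ha.bounds
  -- no temp block (`q = 0`, `m = 0`: the third arm of `LoopSpan` is the empty window at 0), or the block's place
  have htr : (q = 0 ∧ m = 0) ∨ (q % 8 = 0 ∧ A.1.B + A.1.T ≤ q ∧ q + r8 m + 32 ≤ A.1.B + A.1.L) := by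
    rcases hq with hq | hq
    · exact Or.inr (ha.tblock_range hq)
    · exact Or.inl hq
  have hto : (q = 0 ∧ m = 0) ∨ (0x100000 ≤ q ∧ q + m ≤ 0xC00000 ∧ (q + m ≤ 0x700000 ∨ 0x800000 ≤ q)) := by
    rcases hq with hq | hq
    · exact Or.inr (ha.tblock_off hq)
    · exact Or.inl hq
  have hr8 := le_r8 m
  -- a range of the own frame at or above `R` that misses the spill slot reads the same
  have hstack : ∀ lo hi, g.R ≤ lo → hi ≤ g.RA + 8 → (hi ≤ g.R + 0x28 ∨ g.R + 0x30 ≤ lo) → Mem.EqOn lo hi v.mem s.mem := by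
    intro lo hi h1 h2 h3
    apply hs.eqOn
    intro w hw
    have := hws w hw
    unfold LoopSpan OffArena at this
    omega
  have he : ObjEq cfgWins v.mem g.f s.mem g.f := by
    apply ObjEq.of_sameExcept hs
    · intro w hw
      simp only [cfgWins, List.mem_cons, List.mem_nil_iff, or_false] at hw
      rcases hw with rfl | rfl | rfl | rfl | rfl | rfl <;> simp only [] <;> omega
    · intro w hw sp hsp
      have := hws sp hsp
      unfold LoopSpan OffArena at this
      simp only [cfgWins, List.mem_cons, List.mem_nil_iff, or_false] at hw
      rcases hw with rfl | rfl | rfl | rfl | rfl | rfl <;> simp only [] <;> omega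
  have hk : AllKept A.1.Blk v.mem s.mem := by
    apply AllKept.of_sameExcept ha.blkOK hs
    intro B hB w hw
    have h1 := ha.blk_off_stack hB
    have h2 := arena_inside ha hB
    have h3 : (q = 0 ∧ m = 0) ∨ B.disjoint ⟨q, m⟩ := by
      rcases hq with hq | hq
      · exact Or.inr (ha.blk_tblock_disjoint hB hq)
      · exact Or.inl hq
    simp only [vblock] at h3
    have := hws w hw
    unfold LoopSpan OffArena at this
    omega
  have ecb : g.cb s.mem i = g.cb v.mem i := by
    unfold Ghost.cb
    simp only [stb_vorbis.codebooks_at, vacc, voff]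
    rw [he.u64 168 (by decide)]
  have hlog : Log2_4In s.mem := by
    apply log2_carry hfr.sh7 hs
    intro w hw
    have hol := obj_off_log2 hcur.sd.env.ok
    have ho := hcur.hand.outside ⟨0x120640, 16⟩ (by
      simp only [fixedBlocks, globalBlocks, List.mem_cons, Block.mk.injEq, or_true, true_or])
    simp only [] at ho
    have := hws w hw
    unfold LoopSpan OffArena at this
    omega
  have hcur' : Cur g i A2 A3 Ai A s :=
    cur_transport2 hcur hr14 hb hsh (hstack _ _ (by omega) (by omega) (by omega))
      (hstack _ _ (by omega) (by omega) (by omega)) (by omega) he hk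
  have hcb := hcur.ages.cbOK
  have hcbA : A.1.Blk (codebooksBlock v.mem g.f) := hcb.F2.mono hcur.ages.exti
  refine ⟨?_, hcur', Book11.transport hcur hbook ecb hk, ecb,
    Codebook.SameFields.of_kept (hcb.cb_kept (hk _ hcbA) i hcur.lt)⟩
  have e8 := hstack (g.R + 8) (g.R + 16) (by omega) (by omega) (by omega)
  have esv := hstack (g.R + 0x598) (g.R + 0x5d0) (by omega) (by omega) (by omega)
  refine
    { entry := hfr.entry
      rip := rfl
      rsp := hrsp.trans hfr.rsp
      shadowIdx := (e8.u64 (g.R + 8) (by omega) (by omega) (by omega)).trans hfr.shadowIdx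
      saved_rbx := (esv.u64 (g.R + 0x598) (by omega) (by omega) (by omega)).trans hfr.saved_rbx
      saved_rbp := (esv.u64 (g.R + 0x5a0) (by omega) (by omega) (by omega)).trans hfr.saved_rbp
      saved_r12 := (esv.u64 (g.R + 0x5a8) (by omega) (by omega) (by omega)).trans hfr.saved_r12
      saved_r13 := (esv.u64 (g.R + 0x5b0) (by omega) (by omega) (by omega)).trans hfr.saved_r13
      saved_r14 := (esv.u64 (g.R + 0x5b8) (by omega) (by omega) (by omega)).trans hfr.saved_r14
      saved_r15 := (esv.u64 (g.R + 0x5c0) (by omega) (by omega) (by omega)).trans hfr.saved_r15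
      saved_ra := (esv.u64 (g.R + 0x5c8) (by omega) (by omega) (by omega)).trans hfr.saved_ra
      code := hcode
      inv := hinv
      shadow := hfr.shadow.untouched hsh
      offText := hfr.offText
      ext := hfr.ext
      callers := hfr.callers
      sh7 := hlog
      same := ?_ }
  apply hfr.same.trans
  apply hs.mono
  intro w hw a h1 h2
  have := hws w hw
  unfold LoopSpan OffArena at this
  have eB := hfr.ext.B
  have eL := hfr.ext.L
  have hstk : (g.RA - 1888 ≤ w.lo ∧ w.hi ≤ g.RA) → ∃ w', w' ∈ footprint g ∧ w'.lo ≤ a ∧ a < w'.hi := by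
    intro hin
    refine ⟨⟨g.RA - depth, g.RA⟩, List.mem_cons_self, ?_, ?_⟩
    · show g.RA - depth ≤ a
      simp only [depth]
      omega
    · show a < g.RA
      omega
  have hobj : (g.f ≤ w.lo ∧ w.hi ≤ g.f + 1808) → ∃ w', w' ∈ footprint g ∧ w'.lo ≤ a ∧ a < w'.hi := by
    intro hin
    refine ⟨(objBlock (g.e.reg .rdi).toNat).span, List.mem_cons_of_mem _ List.mem_cons_self, ?_, ?_⟩
    · show g.f ≤ a
      omega
    · show a < g.f + Off.sizeof.stb_vorbis
      simp only [Off.sizeof.stb_vorbis]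
      omega
  rcases this with (h0 | h0 | h0 | h0 | h0 | h0) | h0 | h0
  · exact hstk (by omega)
  · exact hobj (by omega)
  · exact hobj (by omega)
  · exact hobj (by omega)
  · exact hobj (by omega)
  · exact hobj (by omega)
  · exact hstk (by omega)
  · have hne : ¬ (q = 0 ∧ m = 0) := by
      intro hz
      omega
    have htr' := htr.resolve_left hne
    have hto' := hto.resolve_left hne
    clear htr hto
    refine ⟨⟨g.A0.1.B, g.A0.1.B + g.A0.1.L⟩, ?_, ?_, ?_⟩
    · unfold footprint writes
      simp only [List.mem_cons, true_or, or_true]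
    · show g.A0.1.B ≤ a
      omega
    · show a < g.A0.1.B + g.A0.1.L
      omega

/-- **`setup_temp_malloc`'s return, BOTH ARMS, for a general successor arena `A'`** (success: `temp_transition`'s pair; failure: `A' = A`,
with the post's `ArenaOK A` and the shadow layer by `ShadowInv.untouched`): the footprint formally contains `temp_offset` and the
arena's shadow on both arms, so the failure arm is no instance of `Mid11.call`. `hblk`: the setup blocks are the same (`rfl` in both
instances). -/
theorem alloc_transition {u₀ : State} {g : Ghost} {i : Nat} {A2 A3 Ai : Arena} {A : Arena × List Obj} {v s : State}
    (h : Mid11 u₀ g i A2 A3 Ai A v) (A' : Arena × List Obj) (hext : A.1.Extends A'.1)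
    (hsub : ∀ o, o ∈ A.2 → o ∈ A'.2) (hblk : g.Blk A' = g.Blk A) (hoffT : ∀ o, o ∈ A'.2 → L.textHi ≤ o.base) {ws : List Span} (hs : Mem.SameExcept ws v.mem s.mem)
    (hws : ∀ w, w ∈ ws → TempSpan g A.1 w)
    (harena : ArenaOK A'.1 A'.2 s.mem g.f)
    (hshadow : ShadowInv A'.2 g.frames' g.R s.mem)
    (hrsp : s.reg .rsp = v.reg .rsp) (hr14 : s.reg .r14 = v.reg .r14) (hcode : CodeOK u₀ s.mem) (hinv : abiInv s) :
    Frame u₀ g s.rip A' s ∧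
      Cur g i A2 A3 Ai A' s ∧
      Book11 g i Ai A' s.mem ∧
      g.cb s.mem i = g.cb v.mem i ∧ Codebook.SameFields v.mem s.mem (g.cb v.mem i) := by
  obtain ⟨hfr, hcur, hbook, hno⟩ := h
  obtain ⟨hw1, hw2, hw3⟩ := obj_where hfr hcur.hand
  obtain ⟨hra1, hra2, hra3⟩ := hfr.ra
  obtain ⟨hr1, hr2⟩ := hfr.r_eq
  simp only [depth, steady] at hra2 hr1
  have ha := hcur.sd.arena
  have hout := hcur.objOut
  simp only [Off.sizeof.stb_vorbis] at hout
  have hbnd := ha.bounds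
  have hstack : ∀ lo hi, g.R ≤ lo → hi ≤ g.RA + 8 → Mem.EqOn lo hi v.mem s.mem := by
    intro lo hi h1 h2
    apply hs.eqOn
    intro w hw
    have := hws w hw
    unfold TempSpan at this
    omega
  have he : ObjEq cfgWinsT v.mem g.f s.mem g.f := by
    apply ObjEq.of_sameExcept hs
    · intro w hw
      simp only [cfgWinsT, List.mem_cons, List.mem_nil_iff, or_false] at hw
      rcases hw with rfl | rfl | rfl | rfl | rfl | rfl <;> simp only [] <;> omega
    · intro w hw sp hsp
      have := hws sp hsp
      unfold TempSpan at this
      simp only [cfgWinsT, List.mem_cons, List.mem_nil_iff, or_false] at hw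
      rcases hw with rfl | rfl | rfl | rfl | rfl | rfl <;> simp only [] <;> omega
  have hk : AllKept A.1.Blk v.mem s.mem := by
    apply AllKept.of_sameExcept ha.blkOK hs
    intro B hB w hw
    have h1 := ha.blk_off_stack hB
    have h2 := arena_inside ha hB
    have := hws w hw
    unfold TempSpan at this
    omega
  have ecbs : stb_vorbis.codebooks s.mem g.f = stb_vorbis.codebooks v.mem g.f := by
    simp only [vacc, voff]
    exact he.u64 168 (by decide)
  have ecnt : stb_vorbis.codebook_count s.mem g.f = stb_vorbis.codebook_count v.mem g.f := by
    simp only [vacc, voff]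
    exact he.i32 160 (by decide)
  have ecb : g.cb s.mem i = g.cb v.mem i := by
    unfold Ghost.cb
    simp only [stb_vorbis.codebooks_at]
    rw [ecbs]
  have hhand : g.Hand A' := HandOK.mono hcur.hand hext hsub
  have hlive : ∀ x, g.Live A x → g.Live A' x := by
    intro x hx
    obtain ⟨o, ho, hb⟩ := hx
    refine ⟨o, ?_, hb⟩
    rcases List.mem_append.mp ho with h1 | h2
    · exact List.mem_append_left _ h1
    · exact List.mem_append_right _ (hsub o h2)
  have hb : Bits (g.Blk A) g.len s.mem g.f := by
    apply hcur.sd.bits.frame_fields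
    apply Bits.SameFields.of_sameExcept hs
    all_goals
      intro w hw
      have := hws w hw
      unfold TempSpan at this
      omega
  have hsd : SDw g.len 3 A' (g.Blk A')
      (g.Live A') s.mem g.f g.R := by
    rw [hblk]
    refine
      { env := ⟨hshadow.shadow.covers, hcur.sd.env.ok, BlkLive.mono hcur.sd.env.live hlive⟩
        frame := hcur.sd.frame.frame (hstack _ _ (by omega) (by omega)) (by omega)
        arena := harena
        setups := fun B hB => by
          rw [← hblk]
          exact up g A' B hB
        bits := hb
        first := ?_
        discard0 := ?_
        header := fun hk' => (hcur.sd.header hk').transfer (he.sub (by decide))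
        cb0 := fun hk' => ⟨(hcur.sd.cb0 hk').1.transfer (he.sub (by decide)) (fun _ _ hB => hB), ?_⟩
        rest := ?_ }
    · have h1 := hcur.sd.first
      simp only [vacc, voff] at h1 ⊢
      rw [he.u8 1749 (by decide)]
      exact h1
    · have h1 := hcur.sd.discard0
      simp only [vacc, voff] at h1 ⊢
      rw [he.i32 1784 (by decide)]
      exact h1
    · rw [ecbs]
      exact (hcur.sd.cb0 hk').2
    · have h1 := hcur.sd.rest
      unfold RestZero restFrom at h1 ⊢
      simp only [voff] at h1 ⊢
      have e : (if 3 ≤ 2 then 160 else if 3 ≤ 5 then 176 else if 3 = 6 then 320 else if 3 = 7 then 464 else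
          if 3 = 8 then 480 else if 3 = 9 then 868 else if 3 = 10 then 1400 else 1480) = 176 := by decide
      rw [e] at h1 ⊢
      intro o ho1 ho2
      have hm : ((144, 1484) : Nat × Nat) ∈ cfgWinsT := by decide
      rw [he (144, 1484) hm o (by simp only []; omega) (by simp only []; omega)]
      exact h1 o ho1 ho2
  have hF1 := hcur.ages.F1
  have hlt := hcur.lt
  have hcb := hcur.ages.cbOK
  have hcbA : A.1.Blk (codebooksBlock v.mem g.f) := hcb.F2.mono hcur.ages.exti
  have hkcb := hk _ hcbA
  have hcur' : Cur g i A2 A3 Ai A' s := by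
    refine
      { sd := hsd
        hand := hhand
        ages := (hcur.ages.frame_old (he.sub (by decide)) (fun B hB => hk B (hB.mono hcur.ages.exti))).grow hext
        zf := ?_
        lt := ?_
        slot_f := ?_
        slot_i := ?_
        r14 := ?_ }
    · rw [ecbs, ecnt]
      have hw := hkcb.inside
      have hsm := hkcb.same
      simp only [vblock] at hw hsm
      apply hcur.zf.same
      · apply Mem.EqOn.mono hsm
        · simp only [voff]
          omega
        · exact Nat.le_refl _
      · omega
      · exact hw
    · rw [ecnt]
      exact hcur.lt
    · rw [← hcur.slot_f]
      exact (hstack (g.R + 0x18) (g.R + 0x20) (by omega) (by omega)).u64 (g.R + 0x18) (by omega) (by omega) (by omega)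
    · rw [← hcur.slot_i]
      exact (hstack (g.R + 0x30) (g.R + 0x34) (by omega) (by omega)).u32 (g.R + 0x30) (by omega) (by omega) (by omega)
    · rw [hr14, ecb]
      exact hcur.r14
  have hbook0 : Book11 g i Ai A s.mem := Book11.transport hcur hbook ecb hk
  have hbook' : Book11 g i Ai A' s.mem :=
    ⟨K15.mono hbook0.k (fun B hB => hB.mono hext), hbook0.type_12, hbook0.prod_le, hbook0.mu0⟩
  have hlog : Log2_4In s.mem := by
    apply log2_carry hfr.sh7 hs
    intro w hw
    have hol := obj_off_log2 hcur.sd.env.ok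
    have := hws w hw
    unfold TempSpan at this
    omega
  refine ⟨?_, hcur', hbook', ecb, Codebook.SameFields.of_kept (hcb.cb_kept hkcb i hcur.lt)⟩
  have e8 := hstack (g.R + 8) (g.R + 16) (by omega) (by omega)
  have esv := hstack (g.R + 0x598) (g.R + 0x5d0) (by omega) (by omega)
  refine
    { entry := hfr.entry
      rip := rfl
      rsp := hrsp.trans hfr.rsp
      shadowIdx := (e8.u64 (g.R + 8) (by omega) (by omega) (by omega)).trans hfr.shadowIdx
      saved_rbx := (esv.u64 (g.R + 0x598) (by omega) (by omega) (by omega)).trans hfr.saved_rbx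
      saved_rbp := (esv.u64 (g.R + 0x5a0) (by omega) (by omega) (by omega)).trans hfr.saved_rbp
      saved_r12 := (esv.u64 (g.R + 0x5a8) (by omega) (by omega) (by omega)).trans hfr.saved_r12
      saved_r13 := (esv.u64 (g.R + 0x5b0) (by omega) (by omega) (by omega)).trans hfr.saved_r13
      saved_r14 := (esv.u64 (g.R + 0x5b8) (by omega) (by omega) (by omega)).trans hfr.saved_r14
      saved_r15 := (esv.u64 (g.R + 0x5c0) (by omega) (by omega) (by omega)).trans hfr.saved_r15
      saved_ra := (esv.u64 (g.R + 0x5c8) (by omega) (by omega) (by omega)).trans hfr.saved_ra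
      code := hcode
      inv := hinv
      shadow := hshadow
      offText := ?_
      ext := hfr.ext.trans hext
      callers := hfr.callers
      sh7 := hlog
      same := ?_ }
  · exact hoffT
  · apply hfr.same.trans
    apply hs.mono
    intro w hw a h1 h2
    have := hws w hw
    unfold TempSpan at this
    have eB := hfr.ext.B
    have eL := hfr.ext.L
    rcases this with h0 | h0 | h0
    · refine ⟨⟨g.RA - depth, g.RA⟩, List.mem_cons_self, ?_, ?_⟩
      · show g.RA - depth ≤ a
        simp only [depth]
        omega
      · show a < g.RA
        omega
    · refine ⟨(objBlock (g.e.reg .rdi).toNat).span, List.mem_cons_of_mem _ List.mem_cons_self, ?_, ?_⟩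
      · show g.f ≤ a
        omega
      · show a < g.f + Off.sizeof.stb_vorbis
        simp only [Off.sizeof.stb_vorbis]
        omega
    · refine ⟨shadowSpan g.A0.1.B (g.A0.1.B + g.A0.1.L), ?_, ?_, ?_⟩
      · unfold footprint writes
        simp only [List.mem_cons, true_or, or_true]
      · show 0xC00000 + g.A0.1.B / 8 ≤ a
        rw [← eB]
        omega
      · show a < 0xC00000 + (g.A0.1.B + g.A0.1.L + 7) / 8
        rw [← eB, ← eL]
        omega

/-- **ERRSTUB(20) of line 3884 (FIX 17), 0x114d41 → 0x113b22**: the five instructions of `stub_3889` at another address. -/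
theorem stub_3884 {Lay : Layout} {μ : Microarch} {u₀ : State} (henv : Env0 Lay μ u₀)
    (h_error : ∀ (others : List Obj) (frames : List (Nat × FrameLayout)),
      Calls Lay μ Vorbis.WayInv (Vorbis.conv u₀) Vorbis.L.error.entry (Vorbis.Spec.error.spec others frames))
    (g : Ghost) (i : Nat) (A2 A3 Ai : Arena) (A : Arena × List Obj) (v : State)
    (hmid : Mid11 u₀ g i A2 A3 Ai A v) (hrip : v.rip = 0x114d41) :
    ReachVia Lay μ WayInv v (fun w => AtERR u₀ g w) := by
  obtain ⟨hLay, hμ, hcode⟩ := henv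
  have he := hmid.fr.entry
  v_entry he
  have w_rip := hrip
  have c_rsp := rsp_form hmid.fr
  have w_eq : Mem.EqOn Vorbis.L.textLo Vorbis.L.textHi u₀.mem v.mem := hmid.fr.code
  have hdf : v.flags .df = false := (show abiInv _ from hmid.fr.inv).1
  have hmx : v.mxcsr &&& 0x1F80 = 0x1F80 := (show abiInv _ from hmid.fr.inv).2
  have hsse := Vorbis.sseOK_of_abiInv hmid.fr.inv
  have sf : v.mem.readLE (g.e.reg .rsp - 1456) 8 = g.f := by
    have e := slot_form hmid.fr 24 1456 (by omega)
    have hs := hmid.cur.slot_f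
    unfold Mem.u64 at hs
    rw [e] at hs
    exact hs
  have herr := h_error A.2 g.frames'
  simp only [depth] at he_room he_stack
  obtain ⟨hw1, hw2, hw3⟩ := obj_where hmid.fr hmid.cur.hand
  unfold Ghost.RA at hw3
  have hfdef : g.f = (g.e.reg .rdi).toNat := rfl
  have hR : g.R = (g.e.reg .rsp).toNat - 1480 := rfl
  u_walk hcode [hμ.vendor] until [Vorbis.L.start_decoder.cut4] span [Vorbis.L.textLo, Vorbis.L.textHi] side (v_side)
  · v_inv
  · -- pre of error(f, 20)
    refine ⟨(call_pre hmid w_mem w_rsp).1, ?_⟩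
    have hrdi : (s_114d4e.reg .rdi).toNat = g.f := by
      rw [w_rdi]
      unfold Ghost.f
      rw [UInt64.ofNat_toNat]
    rw [hrdi]
    exact hmid.cur.hand.obj.mono (sub_frames' g A)
  · v_after_call w_rsp_114d4e w_mem_114d4e
    have c_rdi : s_114d4e.reg .rdi = g.e.reg .rdi := by
      rw [w_rdi_114d4e]
      unfold Ghost.f
      rw [UInt64.ofNat_toNat]
    simp only [c_rdi, voff] at w_same
    obtain ⟨hrax, hunp, _⟩ := w_post
    obtain ⟨_, _, hun0⟩ := call_pre hmid w_mem_114d4e w_rsp_114d4e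
    have hun : ShadowUntouched v.mem s_114d4er.mem := Mem.EqOn.trans hun0 hunp
    have hsame : Mem.SameExcept
        [⟨(g.e.reg .rsp).toNat - 1840, (g.e.reg .rsp).toNat - 1480⟩,
         ⟨(g.e.reg .rdi).toNat + 140, (g.e.reg .rdi).toNat + 144⟩] v.mem s_114d4er.mem := by
      u_same
    have hws : ∀ w, w ∈ [(⟨(g.e.reg .rsp).toNat - 1840, (g.e.reg .rsp).toNat - 1480⟩ : Span),
        ⟨(g.e.reg .rdi).toNat + 140, (g.e.reg .rdi).toNat + 144⟩] → OffArena g w := by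
      intro w hw
      unfold OffArena Ghost.RA
      simp only [List.mem_cons, List.mem_nil_iff, or_false] at hw
      rcases hw with rfl | rfl <;> simp only [] <;> omega
    have hb : Bits (g.Blk A) g.len s_114d4er.mem g.f := by
      apply hmid.cur.sd.bits.frame_fields
      apply Bits.SameFields.of_sameExcept hsame
      all_goals
        intro w hw
        simp only [List.mem_cons, List.mem_nil_iff, or_false] at hw
        rcases hw with rfl | rfl <;> simp only [] <;> omega
    have hmid1 : Mid11 u₀ g i A2 A3 Ai A s_114d4er :=
      hmid.call hsame hws hb hun (w_rsp.trans c_rsp.symm) (w_kept.get .r14 rfl) w_eq w_inv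
    have c_rax : s_114d4er.reg .rax = 0 := hrax
    clear hsame w_same hun hun0 hunp hb
    u_walk hcode [hμ.vendor] until [Vorbis.L.start_decoder.cut4] span [Vorbis.L.textLo, Vorbis.L.textHi] side (v_side)
    -- the common epilogue's entry: `Mid` survives the `jmp`, eax = 0, SD.ERR from CUR(i)
    have hfr : Frame u₀ g pc_ERR A s_114d53 := by
      have h1 : Frame u₀ g s_114d4er.rip A s_114d4er := hmid1.fr
      exact
        { entry := h1.entry
          rip := w_rip
          rsp := by
            rw [w_rsp, ← c_rsp]
            exact hmid.fr.rsp
          shadowIdx := by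
            rw [w_mem]
            exact h1.shadowIdx
          saved_rbx := by
            rw [w_mem]
            exact h1.saved_rbx
          saved_rbp := by
            rw [w_mem]
            exact h1.saved_rbp
          saved_r12 := by
            rw [w_mem]
            exact h1.saved_r12
          saved_r13 := by
            rw [w_mem]
            exact h1.saved_r13
          saved_r14 := by
            rw [w_mem]
            exact h1.saved_r14
          saved_r15 := by
            rw [w_mem]
            exact h1.saved_r15
          saved_ra := by
            rw [w_mem]
            exact h1.saved_ra
          code := w_eq
          inv := by
            refine ⟨?_, ?_⟩
            · rw [w_flags]
              exact w_df
            · rw [w_mxcsr]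
              exact w_mx
          shadow := by
            rw [w_mem]
            exact h1.shadow
          offText := h1.offText
          ext := h1.ext
          callers := h1.callers
          sh7 := by
            rw [w_mem]
            exact h1.sh7
          same := by
            rw [w_mem]
            exact h1.same }
    refine ReachVia.done ⟨A, hfr, hmid1.cur.hand, Or.inl ⟨?_, ?_⟩⟩
    · rw [w_rax]
      rfl
    · rw [w_mem]
      exact hmid1.cur.failed

/-- **ERRSTUB(3) of line 3891 (`mults == NULL`), 0x114d6f → 0x113b22**: the five instructions of `stub_3889` at another address,
`esi = 3` (outofmem). -/
theorem stub_3891 {Lay : Layout} {μ : Microarch} {u₀ : State} (henv : Env0 Lay μ u₀)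
    (h_error : ∀ (others : List Obj) (frames : List (Nat × FrameLayout)),
      Calls Lay μ Vorbis.WayInv (Vorbis.conv u₀) Vorbis.L.error.entry (Vorbis.Spec.error.spec others frames))
    (g : Ghost) (i : Nat) (A2 A3 Ai : Arena) (A : Arena × List Obj) (v : State)
    (hmid : Mid11 u₀ g i A2 A3 Ai A v) (hrip : v.rip = 0x114d6f) :
    ReachVia Lay μ WayInv v (fun w => AtERR u₀ g w) := by
  obtain ⟨hLay, hμ, hcode⟩ := henv
  have he := hmid.fr.entry
  v_entry he
  have w_rip := hrip
  have c_rsp := rsp_form hmid.fr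
  have w_eq : Mem.EqOn Vorbis.L.textLo Vorbis.L.textHi u₀.mem v.mem := hmid.fr.code
  have hdf : v.flags .df = false := (show abiInv _ from hmid.fr.inv).1
  have hmx : v.mxcsr &&& 0x1F80 = 0x1F80 := (show abiInv _ from hmid.fr.inv).2
  have hsse := Vorbis.sseOK_of_abiInv hmid.fr.inv
  have sf : v.mem.readLE (g.e.reg .rsp - 1456) 8 = g.f := by
    have e := slot_form hmid.fr 24 1456 (by omega)
    have hs := hmid.cur.slot_f
    unfold Mem.u64 at hs
    rw [e] at hs
    exact hs
  have herr := h_error A.2 g.frames'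
  simp only [depth] at he_room he_stack
  obtain ⟨hw1, hw2, hw3⟩ := obj_where hmid.fr hmid.cur.hand
  unfold Ghost.RA at hw3
  have hfdef : g.f = (g.e.reg .rdi).toNat := rfl
  have hR : g.R = (g.e.reg .rsp).toNat - 1480 := rfl
  u_walk hcode [hμ.vendor] until [Vorbis.L.start_decoder.cut4] span [Vorbis.L.textLo, Vorbis.L.textHi] side (v_side)
  · v_inv
  · -- pre of error(f, 20)
    refine ⟨(call_pre hmid w_mem w_rsp).1, ?_⟩
    have hrdi : (s_114d7c.reg .rdi).toNat = g.f := by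
      rw [w_rdi]
      unfold Ghost.f
      rw [UInt64.ofNat_toNat]
    rw [hrdi]
    exact hmid.cur.hand.obj.mono (sub_frames' g A)
  · v_after_call w_rsp_114d7c w_mem_114d7c
    have c_rdi : s_114d7c.reg .rdi = g.e.reg .rdi := by
      rw [w_rdi_114d7c]
      unfold Ghost.f
      rw [UInt64.ofNat_toNat]
    simp only [c_rdi, voff] at w_same
    obtain ⟨hrax, hunp, _⟩ := w_post
    obtain ⟨_, _, hun0⟩ := call_pre hmid w_mem_114d7c w_rsp_114d7c
    have hun : ShadowUntouched v.mem s_114d7cr.mem := Mem.EqOn.trans hun0 hunp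
    have hsame : Mem.SameExcept
        [⟨(g.e.reg .rsp).toNat - 1840, (g.e.reg .rsp).toNat - 1480⟩,
         ⟨(g.e.reg .rdi).toNat + 140, (g.e.reg .rdi).toNat + 144⟩] v.mem s_114d7cr.mem := by
      u_same
    have hws : ∀ w, w ∈ [(⟨(g.e.reg .rsp).toNat - 1840, (g.e.reg .rsp).toNat - 1480⟩ : Span),
        ⟨(g.e.reg .rdi).toNat + 140, (g.e.reg .rdi).toNat + 144⟩] → OffArena g w := by
      intro w hw
      unfold OffArena Ghost.RA
      simp only [List.mem_cons, List.mem_nil_iff, or_false] at hw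
      rcases hw with rfl | rfl <;> simp only [] <;> omega
    have hb : Bits (g.Blk A) g.len s_114d7cr.mem g.f := by
      apply hmid.cur.sd.bits.frame_fields
      apply Bits.SameFields.of_sameExcept hsame
      all_goals
        intro w hw
        simp only [List.mem_cons, List.mem_nil_iff, or_false] at hw
        rcases hw with rfl | rfl <;> simp only [] <;> omega
    have hmid1 : Mid11 u₀ g i A2 A3 Ai A s_114d7cr :=
      hmid.call hsame hws hb hun (w_rsp.trans c_rsp.symm) (w_kept.get .r14 rfl) w_eq w_inv
    have c_rax : s_114d7cr.reg .rax = 0 := hrax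
    clear hsame w_same hun hun0 hunp hb
    u_walk hcode [hμ.vendor] until [Vorbis.L.start_decoder.cut4] span [Vorbis.L.textLo, Vorbis.L.textHi] side (v_side)
    -- the common epilogue's entry: `Mid` survives the `jmp`, eax = 0, SD.ERR from CUR(i)
    have hfr : Frame u₀ g pc_ERR A s_114d81 := by
      have h1 : Frame u₀ g s_114d7cr.rip A s_114d7cr := hmid1.fr
      exact
        { entry := h1.entry
          rip := w_rip
          rsp := by
            rw [w_rsp, ← c_rsp]
            exact hmid.fr.rsp
          shadowIdx := by
            rw [w_mem]
            exact h1.shadowIdx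
          saved_rbx := by
            rw [w_mem]
            exact h1.saved_rbx
          saved_rbp := by
            rw [w_mem]
            exact h1.saved_rbp
          saved_r12 := by
            rw [w_mem]
            exact h1.saved_r12
          saved_r13 := by
            rw [w_mem]
            exact h1.saved_r13
          saved_r14 := by
            rw [w_mem]
            exact h1.saved_r14
          saved_r15 := by
            rw [w_mem]
            exact h1.saved_r15
          saved_ra := by
            rw [w_mem]
            exact h1.saved_ra
          code := w_eq
          inv := by
            refine ⟨?_, ?_⟩
            · rw [w_flags]
              exact w_df
            · rw [w_mxcsr]
              exact w_mx
          shadow := by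
            rw [w_mem]
            exact h1.shadow
          offText := h1.offText
          ext := h1.ext
          callers := h1.callers
          sh7 := by
            rw [w_mem]
            exact h1.sh7
          same := by
            rw [w_mem]
            exact h1.same }
    refine ReachVia.done ⟨A, hfr, hmid1.cur.hand, Or.inl ⟨?_, ?_⟩⟩
    · rw [w_rax]
      rfl
    · rw [w_mem]
      exact hmid1.cur.failed

/-- **Leg E0, 0x114c35 → 0x114c49 ∨ 0x114cfb** (C line 3882 `if (c->lookup_type == 1)`: the check, the compare, the branch). r14 is
given to the walker as a Word VARIABLE `cw` with `cw.toNat = c` — with `addr c` the load through the pushed return address stays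
unresolved (`u_omega` does not see through `addr c + 25`). -/
theorem legE0 {Lay : Layout} {μ : Microarch} {u₀ : State} (henv : Env0 Lay μ u₀)
    (hld1 : Asan.SmallCheck Lay μ Vorbis.WayInv (Vorbis.CodeOK u₀) [.rax, .rdx] 1 Vorbis.L.__asan_load1_noabort.entry)
    (g : Ghost) (i : Nat) (A2 A3 Ai : Arena) (A : Arena × List Obj) (v : State)
    (hat : AtPt u₀ g i A2 A3 Ai A 0x114c35 v)
    (hvb : 1 ≤ Codebook.value_bits v.mem (g.cb v.mem i) ∧ Codebook.value_bits v.mem (g.cb v.mem i) ≤ 16) :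
    ReachVia Lay μ WayInv v (fun w =>
      (AtPt u₀ g i A2 A3 Ai A 0x114c49 w ∧ Codebook.lookup_type w.mem (g.cb w.mem i) = 2 ∧ (1 ≤ Codebook.value_bits w.mem (g.cb w.mem i) ∧ Codebook.value_bits w.mem (g.cb w.mem i) ≤ 16)) ∨
      (AtPt u₀ g i A2 A3 Ai A 0x114cfb w ∧ Codebook.lookup_type w.mem (g.cb w.mem i) = 1 ∧ (1 ≤ Codebook.value_bits w.mem (g.cb w.mem i) ∧ Codebook.value_bits w.mem (g.cb w.mem i) ≤ 16))) := by
  obtain ⟨hLay, hμ, hcode⟩ := henv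
  obtain ⟨hmid, hrip, c_r15⟩ := hat
  have he := hmid.fr.entry
  v_entry he
  have w_rip := hrip
  have c_rsp := rsp_form hmid.fr
  have w_eq : Mem.EqOn Vorbis.L.textLo Vorbis.L.textHi u₀.mem v.mem := hmid.fr.code
  have hdf : v.flags .df = false := (show abiInv _ from hmid.fr.inv).1
  have hmx : v.mxcsr &&& 0x1F80 = 0x1F80 := (show abiInv _ from hmid.fr.inv).2
  have hsse := Vorbis.sseOK_of_abiInv hmid.fr.inv
  simp only [depth] at he_room he_stack
  obtain ⟨hc1, hc2, hc3⟩ := cb_where hmid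
  have ht12 := hmid.book.type_12
  obtain ⟨c, hc⟩ : ∃ c, g.cb v.mem i = c := ⟨_, rfl⟩
  rw [hc] at hc1 hc2 hc3 ht12
  obtain ⟨cw, c_r14⟩ : ∃ cw, v.reg .r14 = cw := ⟨_, rfl⟩
  have hcw : cw.toNat = c := by
    rw [← c_r14, hmid.cur.r14, hc]
    exact toNat_addr c (by omega)
  have ecw : cw = addr c := eq_addr cw c hcw
  obtain ⟨lt, hlt⟩ : ∃ lt, Codebook.lookup_type v.mem c = lt := ⟨_, rfl⟩
  rw [hlt] at ht12
  have r19 : v.mem.readLE (cw + 25) 1 = lt := by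
    rw [ecw, ← hlt]
    simp only [vfield, vacc, voff]
  u_walk hcode [hμ.vendor] until [0x114c49, 0x114cfb] span [Vorbis.L.textLo, Vorbis.L.textHi] side (v_side)
  · -- the check of `c->lookup_type`
    have hun : ShadowUntouched v.mem s_114c39.mem := by v_untouched
    refine check_field hmid hun 25 1 (by omega) (by omega) ?_
    rw [hc]
    u_omega
  · -- `lookup_type = 1`: on to 0x114cfb
    have hR : g.R = (g.e.reg .rsp).toNat - 1480 := rfl
    have hsp : Mem.SameExcept [⟨g.RA - 1488, g.RA - 1480⟩] v.mem s_114c43.mem := by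
      rw [w_mem]
      apply Mem.SameExcept.writeLE
      · u_omega
      · refine ⟨_, List.mem_cons_self, ?_, ?_⟩
        · simp only []
          unfold Ghost.RA
          u_omega
        · simp only []
          unfold Ghost.RA
          u_omega
    have hwsp : ∀ w, w ∈ [(⟨g.RA - 1488, g.RA - 1480⟩ : Span)] → OffArena g w := by
      intro w hw
      have e1 := List.mem_singleton.mp hw
      subst e1
      unfold OffArena Ghost.RA
      simp only []
      omega
    have hp := hmid.push 1133630
    have hb : Bits (g.Blk A) g.len s_114c43.mem g.f := by
      rw [w_mem]
      exact hp.cur.sd.bits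
    have hsh : ShadowUntouched v.mem s_114c43.mem := by
      rw [w_mem]
      exact Mem.eqOn_writeLE v.mem _ 8 _ 0xC00000 0x200000 (by u_omega) (by u_omega)
    have hinv : abiInv s_114c43 := by
      refine ⟨?_, ?_⟩
      · rw [w_flags]
        simp only [X86.User.df_setStatus]
        exact w_df_114c39
      · rw [w_mxcsr]
        exact hmx
    have hm : Mid11 u₀ g i A2 A3 Ai A s_114c43 :=
      hmid.call hsp hwsp hb hsh (w_rsp.trans c_rsp.symm) (w_kept.get .r14 rfl) w_eq hinv
    obtain ⟨ecb, esf⟩ := call_fields hmid hsp hwsp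
    have elt : Codebook.lookup_type s_114c43.mem (g.cb s_114c43.mem i) = lt := by
      rw [ecb, esf.lookup_type, hc]
      exact hlt
    have hr15 : s_114c43.reg .r15 = addr g.f := by
      rw [w_kept.get .r15 rfl]
      exact c_r15
    refine ReachVia.done (Or.inr ⟨⟨hm, w_rip, hr15⟩, ?_, ?_⟩)
    · rw [elt]
      omega
    · rw [ecb, esf.value_bits]
      exact hvb
  · -- `lookup_type = 2`: on to 0x114c49
    have hR : g.R = (g.e.reg .rsp).toNat - 1480 := rfl
    have hsp : Mem.SameExcept [⟨g.RA - 1488, g.RA - 1480⟩] v.mem s_114c43.mem := by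
      rw [w_mem]
      apply Mem.SameExcept.writeLE
      · u_omega
      · refine ⟨_, List.mem_cons_self, ?_, ?_⟩
        · simp only []
          unfold Ghost.RA
          u_omega
        · simp only []
          unfold Ghost.RA
          u_omega
    have hwsp : ∀ w, w ∈ [(⟨g.RA - 1488, g.RA - 1480⟩ : Span)] → OffArena g w := by
      intro w hw
      have e1 := List.mem_singleton.mp hw
      subst e1
      unfold OffArena Ghost.RA
      simp only []
      omega
    have hp := hmid.push 1133630
    have hb : Bits (g.Blk A) g.len s_114c43.mem g.f := by
      rw [w_mem]
      exact hp.cur.sd.bits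
    have hsh : ShadowUntouched v.mem s_114c43.mem := by
      rw [w_mem]
      exact Mem.eqOn_writeLE v.mem _ 8 _ 0xC00000 0x200000 (by u_omega) (by u_omega)
    have hinv : abiInv s_114c43 := by
      refine ⟨?_, ?_⟩
      · rw [w_flags]
        simp only [X86.User.df_setStatus]
        exact w_df_114c39
      · rw [w_mxcsr]
        exact hmx
    have hm : Mid11 u₀ g i A2 A3 Ai A s_114c43 :=
      hmid.call hsp hwsp hb hsh (w_rsp.trans c_rsp.symm) (w_kept.get .r14 rfl) w_eq hinv
    obtain ⟨ecb, esf⟩ := call_fields hmid hsp hwsp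
    have elt : Codebook.lookup_type s_114c43.mem (g.cb s_114c43.mem i) = lt := by
      rw [ecb, esf.lookup_type, hc]
      exact hlt
    have hr15 : s_114c43.reg .r15 = addr g.f := by
      rw [w_kept.get .r15 rfl]
      exact c_r15
    refine ReachVia.done (Or.inl ⟨⟨hm, w_rip, hr15⟩, ?_, ?_⟩)
    · rw [elt]
      omega
    · rw [ecb, esf.value_bits]
      exact hvb

/-- **Leg E2, 0x114c49 → 0x114c6f** (C line 3887, a type-2 book: `c->lookup_values = c->entries * c->dimensions`): three check
sites, the 32-bit `imul` (exact: FIX 3 bounds the product by 1FFFFFFFH), the store. -/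
theorem legE2 {Lay : Layout} {μ : Microarch} {u₀ : State} (henv : Env0 Lay μ u₀)
    (hst4 : Asan.SmallCheck Lay μ Vorbis.WayInv (Vorbis.CodeOK u₀) [.rax, .rcx, .rdx] 4 Vorbis.L.__asan_store4_noabort.entry)
    (hld4 : Asan.SmallCheck Lay μ Vorbis.WayInv (Vorbis.CodeOK u₀) [.rax, .rcx, .rdx] 4 Vorbis.L.__asan_load4_noabort.entry)
    (g : Ghost) (i : Nat) (A2 A3 Ai : Arena) (A : Arena × List Obj) (v : State)
    (hat : AtPt u₀ g i A2 A3 Ai A 0x114c49 v) (hlt2 : Codebook.lookup_type v.mem (g.cb v.mem i) = 2)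
    (hvb : 1 ≤ Codebook.value_bits v.mem (g.cb v.mem i) ∧ Codebook.value_bits v.mem (g.cb v.mem i) ≤ 16) :
    ReachVia Lay μ WayInv v (fun w => AtPt u₀ g i A2 A3 Ai A 0x114c6f w ∧
      (Codebook.lookup_values w.mem (g.cb w.mem i) : Int) =
        Codebook.entries w.mem (g.cb w.mem i) * Codebook.dimensions w.mem (g.cb w.mem i) ∧ (1 ≤ Codebook.value_bits w.mem (g.cb w.mem i) ∧ Codebook.value_bits w.mem (g.cb w.mem i) ≤ 16) ∧
      Codebook.lookup_type w.mem (g.cb w.mem i) = 2) := by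
  obtain ⟨hLay, hμ, hcode⟩ := henv
  obtain ⟨hmid, hrip, c_r15⟩ := hat
  have he := hmid.fr.entry
  v_entry he
  have w_rip := hrip
  have c_rsp := rsp_form hmid.fr
  have w_eq : Mem.EqOn Vorbis.L.textLo Vorbis.L.textHi u₀.mem v.mem := hmid.fr.code
  have hdf : v.flags .df = false := (show abiInv _ from hmid.fr.inv).1
  have hmx : v.mxcsr &&& 0x1F80 = 0x1F80 := (show abiInv _ from hmid.fr.inv).2
  have hsse := Vorbis.sseOK_of_abiInv hmid.fr.inv
  simp only [depth] at he_room he_stack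
  obtain ⟨hc1, hc2, hc3⟩ := cb_where hmid
  obtain ⟨c, hc⟩ : ∃ c, g.cb v.mem i = c := ⟨_, rfl⟩
  rw [hc] at hc1 hc2 hc3
  obtain ⟨cw, c_r14⟩ : ∃ cw, v.reg .r14 = cw := ⟨_, rfl⟩
  have hcw : cw.toNat = c := by
    rw [← c_r14, hmid.cur.r14, hc]
    exact toNat_addr c (by omega)
  have ecw : cw = addr c := eq_addr cw c hcw
  obtain ⟨en, hen⟩ : ∃ en, v.mem.readLE (cw + 4) 4 = en := ⟨_, rfl⟩
  obtain ⟨dm, hdm⟩ : ∃ dm, v.mem.readLE cw 4 = dm := ⟨_, rfl⟩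
  u_walk hcode [hμ.vendor] until [0x114c6f] span [Vorbis.L.textLo, Vorbis.L.textHi] side (v_side)
  · have hun : ShadowUntouched v.mem s_114c4d.mem := by v_untouched
    refine check_field hmid hun 4 4 (by omega) (by omega) ?_
    rw [hc]
    u_omega
  · have hun : ShadowUntouched v.mem s_114c59.mem := by v_untouched
    refine check_field hmid hun 0 4 (by omega) (by omega) ?_
    rw [hc]
    u_omega
  · have hun : ShadowUntouched v.mem s_114c66.mem := by v_untouched
    refine check_field hmid hun 28 4 (by omega) (by omega) ?_
    rw [hc]
    u_omega
  · -- `Mid11` after the store, and the value stored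
    have hp := hmid.push 1133675
    obtain ⟨hp1, hp2, hp3⟩ := cb_where hp
    dsimp only at hp1 hp2 hp3
    have ec : g.cb (v.mem.writeLE (g.e.reg Reg.rsp - 1488) 8 1133675) i = c := by
      have h1 := hp.cur.r14
      have h2 : addr (g.cb (v.mem.writeLE (g.e.reg Reg.rsp - 1488) 8 1133675) i) = addr c :=
        h1.symm.trans (c_r14.trans ecw)
      exact addr_inj _ _ (by omega) (by omega) h2
    rw [ecw] at w_mem
    simp only [vfield] at w_mem
    have hinv : abiInv s_114c6b := by
      refine ⟨?_, ?_⟩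
      · rw [w_flags]
        exact w_df_114c66
      · rw [w_mxcsr]
        exact hmx
    have hm : Mid11 u₀ g i A2 A3 Ai A s_114c6b := by
      refine hp.store_field (b := c + 28) (k := 4) w_mem ?_ (w_rsp.trans c_rsp.symm) (w_kept.get .r14 rfl) w_eq hinv
      right
      right
      rw [ec]
      omega
    obtain ⟨hq1, hq2, hq3⟩ := cb_where hm
    have ec' : g.cb s_114c6b.mem i = c := by
      have h1 := hm.cur.r14
      have h2 : addr (g.cb s_114c6b.mem i) = addr c := h1.symm.trans ((w_kept.get .r14 rfl).trans (c_r14.trans ecw))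
      exact addr_inj _ _ (by omega) (by omega) h2
    -- the fields read: `entries`, `dimensions` are the two words loaded, non-negative by K1
    have hk1 := hmid.book.k.k1
    have hpl := hmid.book.prod_le
    rw [hc] at hk1 hpl
    have een : Codebook.entries v.mem c = sint32 en := by
      simp only [vacc, voff]
      unfold Mem.i32 Mem.u32
      rw [← hen, ecw]
      simp only [vfield]
    have edm : Codebook.dimensions v.mem c = sint32 dm := by
      simp only [vacc, voff, Nat.add_zero]
      unfold Mem.i32 Mem.u32
      rw [← hdm, ecw]
    have k1a := hk1.ent_nonneg
    have k1b := hk1.ent_lt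
    have k1c := hk1.dim_pos
    have k1d := hk1.dim_le
    rw [een] at k1a k1b hpl
    rw [edm] at k1c k1d hpl
    have b1 : en < 256 ^ 4 := by
      rw [← hen]
      exact Mem.readLE_lt' v.mem _ 4
    have b2 : dm < 256 ^ 4 := by
      rw [← hdm]
      exact Mem.readLE_lt' v.mem _ 4
    have c1 := sint32_cases en
    have c2 := sint32_cases dm
    have hen' : sint32 en = (en : Int) := by omega
    have hdm' : sint32 dm = (dm : Int) := by omega
    rw [hen', hdm'] at hpl
    have hprod : en * dm ≤ 0x1FFFFFFF := by
      have : ((en * dm : Nat) : Int) ≤ 0x1FFFFFFF := by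
        rw [Int.natCast_mul]
        exact hpl
      omega
    have hmul : (BitVec.ofNat 32 en * BitVec.ofNat 32 dm).toNat = en * dm := by
      rw [BitVec.toNat_mul, BitVec.toNat_ofNat, BitVec.toNat_ofNat]
      have h1 : en % 2 ^ 32 = en := Nat.mod_eq_of_lt (by omega)
      have h2 : dm % 2 ^ 32 = dm := Nat.mod_eq_of_lt (by omega)
      rw [h1, h2]
      exact Nat.mod_eq_of_lt (by omega)
    -- the three fields in the final memory
    have hsk : SameK (v.mem.writeLE (g.e.reg Reg.rsp - 1488) 8 1133675) s_114c6b.mem c := by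
      rw [w_mem]
      exact SameK.of_writeLE _ c (c + 28) 4 _ (by omega) (by omega)
    have hR : g.R = (g.e.reg .rsp).toNat - 1480 := rfl
    have hsp : Mem.SameExcept [⟨g.RA - 1488, g.RA - 1480⟩] v.mem (v.mem.writeLE (g.e.reg .rsp - 1488) 8 1133675) := by
      apply Mem.SameExcept.writeLE
      · u_omega
      · refine ⟨_, List.mem_cons_self, ?_, ?_⟩
        · simp only []
          unfold Ghost.RA
          u_omega
        · simp only []
          unfold Ghost.RA
          u_omega
    have hwsp : ∀ w, w ∈ [(⟨g.RA - 1488, g.RA - 1480⟩ : Span)] → OffArena g w := by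
      intro w hw
      have e1 := List.mem_singleton.mp hw
      subst e1
      unfold OffArena Ghost.RA
      simp only []
      omega
    obtain ⟨_, esf⟩ := call_fields hmid hsp hwsp
    rw [hc] at esf
    have e_ent : Codebook.entries s_114c6b.mem c = (en : Int) := by
      have e1 : Codebook.entries s_114c6b.mem c =
          Codebook.entries (v.mem.writeLE (g.e.reg Reg.rsp - 1488) 8 1133675) c := by
        simp only [vacc, voff]
        exact hsk.lo.i32 _ (by omega) (by omega) (by omega)
      rw [e1, esf.entries, een, hen']
    have e_dim : Codebook.dimensions s_114c6b.mem c = (dm : Int) := by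
      have e1 : Codebook.dimensions s_114c6b.mem c =
          Codebook.dimensions (v.mem.writeLE (g.e.reg Reg.rsp - 1488) 8 1133675) c := by
        simp only [vacc, voff]
        exact hsk.lo.i32 _ (by omega) (by omega) (by omega)
      rw [e1, esf.dimensions, edm, hdm']
    have e_lv : Codebook.lookup_values s_114c6b.mem c = en * dm := by
      simp only [vacc, voff]
      unfold Mem.u32
      rw [w_mem, Mem.readLE_writeLE_same _ _ 4 _ (by omega), hmul]
      exact Nat.mod_eq_of_lt (by omega)
    have evb : Codebook.value_bits s_114c6b.mem c = Codebook.value_bits v.mem c := by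
      rw [w_mem, store_keeps_vb _ c (c + 28) 4 _ (by omega) (by omega) (by omega) (by omega)]
      exact esf.value_bits
    have e_lt : Codebook.lookup_type s_114c6b.mem c = 2 := by
      have e1 : Codebook.lookup_type s_114c6b.mem c =
          Codebook.lookup_type (v.mem.writeLE (g.e.reg Reg.rsp - 1488) 8 1133675) c := by
        simp only [vacc, voff]
        exact hsk.lt.u8 _ (by omega) (by omega) (by omega)
      rw [e1, esf.lookup_type, ← hc]
      exact hlt2
    refine ReachVia.done ⟨⟨hm, w_rip, ?_⟩, ?_, ?_, ?_⟩
    · rw [w_kept.get .r15 rfl]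
      exact c_r15
    · rw [ec', e_lv, e_ent, e_dim, Int.natCast_mul]
    · rw [ec', evb, ← hc]
      exact hvb
    · rw [ec', e_lt]

/-- **Leg E1a, 0x114cfb → 0x114d1a** (`cut159`; C line 3883 of a type-1 book up to the return of `lookup1_values(c->entries,
c->dimensions)`): two check sites, the call (an arbitrary int comes back); `lookup_type = 1` is carried. -/
theorem legE1a {Lay : Layout} {μ : Microarch} {u₀ : State} (henv : Env0 Lay μ u₀)
    (hld4 : Asan.SmallCheck Lay μ Vorbis.WayInv (Vorbis.CodeOK u₀) [.rax, .rcx, .rdx] 4 Vorbis.L.__asan_load4_noabort.entry)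
    (h_l1v : ∀ (others : List Obj) (frames : List (Nat × FrameLayout)),
      Calls Lay μ Vorbis.WayInv (Vorbis.conv u₀) Vorbis.L.lookup1_values.entry (Vorbis.Spec.lookup1_values.spec others frames))
    (g : Ghost) (i : Nat) (A2 A3 Ai : Arena) (A : Arena × List Obj) (v : State)
    (hat : AtPt u₀ g i A2 A3 Ai A 0x114cfb v) (hlt1 : Codebook.lookup_type v.mem (g.cb v.mem i) = 1)
    (hvb : 1 ≤ Codebook.value_bits v.mem (g.cb v.mem i) ∧ Codebook.value_bits v.mem (g.cb v.mem i) ≤ 16) :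
    ReachVia Lay μ WayInv v (fun w => AtPt u₀ g i A2 A3 Ai A Vorbis.L.start_decoder.cut159 w ∧
      Codebook.lookup_type w.mem (g.cb w.mem i) = 1 ∧ (1 ≤ Codebook.value_bits w.mem (g.cb w.mem i) ∧ Codebook.value_bits w.mem (g.cb w.mem i) ≤ 16)) := by
  obtain ⟨hLay, hμ, hcode⟩ := henv
  obtain ⟨hmid, hrip, c_r15⟩ := hat
  have he := hmid.fr.entry
  v_entry he
  have w_rip := hrip
  have c_rsp := rsp_form hmid.fr
  have w_eq : Mem.EqOn Vorbis.L.textLo Vorbis.L.textHi u₀.mem v.mem := hmid.fr.code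
  have hdf : v.flags .df = false := (show abiInv _ from hmid.fr.inv).1
  have hmx : v.mxcsr &&& 0x1F80 = 0x1F80 := (show abiInv _ from hmid.fr.inv).2
  have hsse := Vorbis.sseOK_of_abiInv hmid.fr.inv
  simp only [depth] at he_room he_stack
  have hR : g.R = (g.e.reg .rsp).toNat - 1480 := rfl
  obtain ⟨hc1, hc2, hc3⟩ := cb_where hmid
  obtain ⟨c, hc⟩ : ∃ c, g.cb v.mem i = c := ⟨_, rfl⟩
  rw [hc] at hc1 hc2 hc3
  obtain ⟨cw, c_r14⟩ : ∃ cw, v.reg .r14 = cw := ⟨_, rfl⟩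
  have hcw : cw.toNat = c := by
    rw [← c_r14, hmid.cur.r14, hc]
    exact toNat_addr c (by omega)
  obtain ⟨en, hen⟩ : ∃ en, v.mem.readLE (cw + 4) 4 = en := ⟨_, rfl⟩
  obtain ⟨dm, hdm⟩ : ∃ dm, v.mem.readLE cw 4 = dm := ⟨_, rfl⟩
  have hl1 := h_l1v A.2 g.frames'
  u_walk hcode [hμ.vendor] until [Vorbis.L.start_decoder.cut159] span [Vorbis.L.textLo, Vorbis.L.textHi] side (v_side)
  · have hun : ShadowUntouched v.mem s_114cfe.mem := by v_untouched
    refine check_field hmid hun 0 4 (by omega) (by omega) ?_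
    rw [hc]
    u_omega
  · have hun : ShadowUntouched v.mem s_114d0a.mem := by v_untouched
    refine check_field hmid hun 4 4 (by omega) (by omega) ?_
    rw [hc]
    u_omega
  · v_inv
  · -- pre of lookup1_values
    exact (call_pre hmid w_mem w_rsp).1
  · v_after_call w_rsp_114d15 w_mem_114d15
    obtain ⟨_, _, hun0⟩ := call_pre hmid w_mem_114d15 w_rsp_114d15
    have hun : ShadowUntouched v.mem s_114d15r.mem := Mem.EqOn.trans hun0 w_post
    have hsame : Mem.SameExcept [⟨(g.e.reg .rsp).toNat - 1840, (g.e.reg .rsp).toNat - 1480⟩]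
        v.mem s_114d15r.mem := by
      u_same
    have hws : ∀ w, w ∈ [(⟨(g.e.reg .rsp).toNat - 1840, (g.e.reg .rsp).toNat - 1480⟩ : Span)] → OffArena g w := by
      intro w hw
      unfold OffArena Ghost.RA
      have e1 := List.mem_singleton.mp hw
      subst e1
      simp only []
      omega
    obtain ⟨hw1, hw2, hw3⟩ := obj_where hmid.fr hmid.cur.hand
    unfold Ghost.RA at hw3
    have hb2 : Bits (g.Blk A) g.len s_114d15r.mem g.f := by
      apply bits_off hmid.cur.sd.bits hsame
      intro w hw
      have e1 := List.mem_singleton.mp hw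
      subst e1
      simp only []
      omega
    have hmid2 : Mid11 u₀ g i A2 A3 Ai A s_114d15r :=
      hmid.call hsame hws hb2 hun (w_rsp.trans c_rsp.symm) (w_kept.get .r14 rfl) w_eq w_inv
    obtain ⟨ecb, esf⟩ := call_fields hmid hsame hws
    refine ReachVia.done ⟨⟨hmid2, w_rip, ?_⟩, ?_, ?_⟩
    · rw [w_kept.get .r15 rfl]
      exact c_r15
    · rw [ecb, esf.lookup_type]
      exact hlt1
    · rw [ecb, esf.value_bits]
      exact hvb

/-- What the segment establishes about `lookup_values` by 0x114c6f (PROPOSED exit of sub-unit C11b, entry of C11c): `value_bits ∈ [1, 16]`,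
type 1: `0 ≤ LV ≤ entries` as C ints (FIX 17); type 2: `LV = entries · dimensions` (`legE2` proves this clause). -/
structure LVFacts (mem : Mem) (c : Nat) : Prop where
  vb : 1 ≤ Codebook.value_bits mem c ∧ Codebook.value_bits mem c ≤ 16
  type1_lv : Codebook.lookup_type mem c = 1 → (Codebook.lookup_values mem c : Int) ≤ Codebook.entries mem c
  type2_lv : Codebook.lookup_type mem c = 2 →
    (Codebook.lookup_values mem c : Int) = Codebook.entries mem c * Codebook.dimensions mem c

/-- **PROPOSED assertion at 0x114c6f** (exit of C11b, entry of C11c): `AtPt` and `LVFacts`. -/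
def AtLV (u₀ : State) (g : Ghost) (i : Nat) (A2 A3 Ai : Arena) (A : Arena × List Obj) (s : State) : Prop :=
  AtPt u₀ g i A2 A3 Ai A 0x114c6f s ∧ LVFacts s.mem (g.cb s.mem i)

/-- **PROPOSED assertion at the head of loop 3892, `cut157` = 0x114ca3** (exit of C11c with `j = 0`, invariant of C11d; measure
`lookup_values − j`): the conclusion of `alloc_transition` / `trip_transport` (the common part `Frame`, CUR(i), the book under
construction — for the arena WITH the temp block), `Mults` (P4 = the only temp block, its spill slot, `1 ≤ LV < 2^30`), `LVFacts`,
ebp = j ≤ LV. At the exit `jle` (`LV ≤ j`, so `j = LV`) it gives `InC12` field by field: `rbx` is the `LV` just loaded. -/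
structure AtHead11 (u₀ : State) (g : Ghost) (i : Nat) (A2 A3 Ai : Arena) (A : Arena × List Obj) (mults j : Nat) (s : State) :
    Prop where
  fr : Frame u₀ g s.rip A s
  rip : s.rip = Vorbis.L.start_decoder.cut157
  cur : Cur g i A2 A3 Ai A s
  book : Book11 g i Ai A s.mem
  mults : Mults g A s.mem (g.cb s.mem i) mults
  lv : LVFacts s.mem (g.cb s.mem i)
  rbp : s.reg .rbp = addr j
  j_le : j ≤ Codebook.lookup_values s.mem (g.cb s.mem i)

/-- **The proposed loop-head assertion is strong enough for the segment's exit**: with `rip` at `cut165`, `rbx = LV`, it IS `InC12`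
(so no clause of `InC12` is missing from the proposal). -/
theorem AtHead11.toInC12 {u₀ : State} {g : Ghost} {i : Nat} {A2 A3 Ai : Arena} {A : Arena × List Obj} {mults j : Nat} {s : State}
    (h : AtHead11 u₀ g i A2 A3 Ai A mults j s) (hfr : Frame u₀ g pc_C12 A s)
    (hrbx : s.reg .rbx = addr (Codebook.lookup_values s.mem (g.cb s.mem i))) : InC12 u₀ g i A2 A3 Ai A mults s :=
  { frame := hfr
    cur := h.cur
    k := h.book.k
    type_12 := h.book.type_12
    prod_le := h.book.prod_le
    rbx := hrbx
    mults := h.mults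
    type1_lv := h.lv.type1_lv
    type2_lv := h.lv.type2_lv
    vb := h.lv.vb
    mu0 := h.book.mu0 }

/-- `Mid11` at a state with the same memory, stack pointer and r14. -/
theorem Mid11.same_mem {u₀ : State} {g : Ghost} {i : Nat} {A2 A3 Ai : Arena} {A : Arena × List Obj} {v s : State}
    (h : Mid11 u₀ g i A2 A3 Ai A v) (hm : s.mem = v.mem) (hrsp : s.reg .rsp = v.reg .rsp)
    (hr14 : s.reg .r14 = v.reg .r14) (hcode : CodeOK u₀ s.mem) (hinv : abiInv s) : Mid11 u₀ g i A2 A3 Ai A s := by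
  have hs : Mem.SameExcept [] v.mem s.mem := by
    rw [hm]
    exact Mem.SameExcept.refl _ _
  have hb : Bits (g.Blk A) g.len s.mem g.f := by
    rw [hm]
    exact h.cur.sd.bits
  have hsh : ShadowUntouched v.mem s.mem := by
    rw [hm]
    exact Mem.EqOn.refl _ _ _
  exact h.call hs (fun w hw => absurd hw List.not_mem_nil) hb hsh hrsp hr14 hcode hinv

/-- `Mid11` at a state whose memory is that of `v` with one word pushed at `[R − 8]` (the return address of a check call). -/
theorem Mid11.pushed {u₀ : State} {g : Ghost} {i : Nat} {A2 A3 Ai : Arena} {A : Arena × List Obj} {v s : State}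
    (h : Mid11 u₀ g i A2 A3 Ai A v) {y : Nat} (hm : s.mem = v.mem.writeLE (g.e.reg .rsp - 1488) 8 y)
    (hrsp : s.reg .rsp = v.reg .rsp) (hr14 : s.reg .r14 = v.reg .r14) (hcode : CodeOK u₀ s.mem) (hinv : abiInv s) :
    Mid11 u₀ g i A2 A3 Ai A s :=
  (h.push y).same_mem (s := s) hm hrsp hr14 hcode hinv

/-- FIX 17 as arithmetic: `test eax, eax ; js` not taken and `cmp [entries], ebx ; jl` not taken give `values ≤ entries`. -/
theorem fix17_le (x : BitVec 32) (en : Nat) (hen : en < 2 ^ 24) (h1 : x.msb = false)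
    (h2 : ¬ (BitVec.ofNat 32 en).toInt < x.toInt) : x.toNat ≤ en := by
  rw [BitVec.toInt_eq_toNat_cond, BitVec.toInt_eq_toNat_cond, BitVec.toNat_ofNat] at h2
  have e : en % 2 ^ 32 = en := Nat.mod_eq_of_lt (by omega)
  rw [e] at h2
  rw [BitVec.msb_eq_decide] at h1
  have h3 : ¬ 2 ^ 31 ≤ x.toNat := by
    intro h
    simp only [h, decide_true] at h1
    exact Bool.noConfusion h1
  split at h2 <;> split at h2 <;> omega

/-- **Leg E1b, 0x114d1a → 0x114c6f ∨ 0x114d41** (`cut159`; C lines 3884 – 3885 of a type-1 book). -/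
theorem legE1b {Lay : Layout} {μ : Microarch} {u₀ : State} (henv : Env0 Lay μ u₀)
    (hst4 : Asan.SmallCheck Lay μ Vorbis.WayInv (Vorbis.CodeOK u₀) [.rax, .rcx, .rdx] 4 Vorbis.L.__asan_store4_noabort.entry)
    (hld4 : Asan.SmallCheck Lay μ Vorbis.WayInv (Vorbis.CodeOK u₀) [.rax, .rcx, .rdx] 4 Vorbis.L.__asan_load4_noabort.entry)
    (g : Ghost) (i : Nat) (A2 A3 Ai : Arena) (A : Arena × List Obj) (v : State)
    (hat : AtPt u₀ g i A2 A3 Ai A Vorbis.L.start_decoder.cut159 v)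
    (hlt1 : Codebook.lookup_type v.mem (g.cb v.mem i) = 1)
    (hvb : 1 ≤ Codebook.value_bits v.mem (g.cb v.mem i) ∧ Codebook.value_bits v.mem (g.cb v.mem i) ≤ 16) :
    ReachVia Lay μ WayInv v (fun w => AtLV u₀ g i A2 A3 Ai A w ∨
      (Mid11 u₀ g i A2 A3 Ai A w ∧ w.rip = 0x114d41)) := by
  obtain ⟨hLay, hμ, hcode⟩ := henv
  obtain ⟨hmid, hrip, c_r15⟩ := hat
  have he := hmid.fr.entry
  v_entry he
  have w_rip := hrip
  have c_rsp := rsp_form hmid.fr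
  have w_eq : Mem.EqOn Vorbis.L.textLo Vorbis.L.textHi u₀.mem v.mem := hmid.fr.code
  have hdf : v.flags .df = false := (show abiInv _ from hmid.fr.inv).1
  have hmx : v.mxcsr &&& 0x1F80 = 0x1F80 := (show abiInv _ from hmid.fr.inv).2
  have hsse := Vorbis.sseOK_of_abiInv hmid.fr.inv
  simp only [depth] at he_room he_stack
  obtain ⟨hc1, hc2, hc3⟩ := cb_where hmid
  obtain ⟨c, hc⟩ : ∃ c, g.cb v.mem i = c := ⟨_, rfl⟩
  rw [hc] at hc1 hc2 hc3
  obtain ⟨cw, c_r14⟩ : ∃ cw, v.reg .r14 = cw := ⟨_, rfl⟩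
  have hcw : cw.toNat = c := by
    rw [← c_r14, hmid.cur.r14, hc]
    exact toNat_addr c (by omega)
  have ecw : cw = addr c := eq_addr cw c hcw
  obtain ⟨en, hen⟩ : ∃ en, v.mem.readLE (cw + 4) 4 = en := ⟨_, rfl⟩
  obtain ⟨z, c_rax⟩ : ∃ z, v.reg .rax = z := ⟨_, rfl⟩
  u_walk hcode [hμ.vendor] until [0x114c6f, 0x114d41] span [Vorbis.L.textLo, Vorbis.L.textHi] side (v_side)
  · -- the check of `c->entries` (FIX 17)
    have hun : ShadowUntouched v.mem s_114d24.mem := by v_untouched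
    refine check_field hmid hun 4 4 (by omega) (by omega) ?_
    rw [hc]
    u_omega
  · -- the check of `c->lookup_values`
    have hun : ShadowUntouched v.mem s_114d33.mem := by v_untouched
    refine check_field hmid hun 28 4 (by omega) (by omega) ?_
    rw [hc]
    u_omega
  · -- `values < 0`: to the error stub
    have hinv : abiInv s_114d1e := by
      refine ⟨?_, ?_⟩
      · rw [w_flags]
        simp only [X86.User.df_setStatus]
        exact hdf
      · rw [w_mxcsr]
        exact hmx
    have hm : Mid11 u₀ g i A2 A3 Ai A s_114d1e :=
      hmid.same_mem w_mem (w_kept.get .rsp rfl) (w_kept.get .r14 rfl) w_eq hinv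
    exact ReachVia.done (Or.inr ⟨hm, w_rip⟩)
  · -- `values > entries`: to the error stub
    have hinv : abiInv s_114d2d := by
      refine ⟨?_, ?_⟩
      · rw [w_flags]
        simp only [X86.User.df_setStatus]
        exact w_df_114d24
      · rw [w_mxcsr]
        exact hmx
    have hm : Mid11 u₀ g i A2 A3 Ai A s_114d2d :=
      hmid.pushed w_mem (w_rsp.trans c_rsp.symm) (w_kept.get .r14 rfl) w_eq hinv
    exact ReachVia.done (Or.inr ⟨hm, w_rip⟩)
  · -- the store of `lookup_values`
    have hp := hmid.push 1133880
    obtain ⟨hp1, hp2, hp3⟩ := cb_where hp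
    dsimp only at hp1 hp2 hp3
    have ec : g.cb (v.mem.writeLE (g.e.reg Reg.rsp - 1488) 8 1133880) i = c := by
      have h1 := hp.cur.r14
      have h2 : addr (g.cb (v.mem.writeLE (g.e.reg Reg.rsp - 1488) 8 1133880) i) = addr c :=
        h1.symm.trans (c_r14.trans ecw)
      exact addr_inj _ _ (by omega) (by omega) h2
    rw [ecw] at w_mem
    simp only [vfield] at w_mem
    have hinv : abiInv s_114d3c := by
      refine ⟨?_, ?_⟩
      · rw [w_flags]
        exact w_df_114d33
      · rw [w_mxcsr]
        exact hmx
    have hm : Mid11 u₀ g i A2 A3 Ai A s_114d3c := by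
      refine hp.store_field (b := c + 28) (k := 4) w_mem ?_ (w_rsp.trans c_rsp.symm) (w_kept.get .r14 rfl) w_eq hinv
      right
      right
      rw [ec]
      omega
    obtain ⟨hq1, hq2, hq3⟩ := cb_where hm
    have ec' : g.cb s_114d3c.mem i = c := by
      have h1 := hm.cur.r14
      have h2 : addr (g.cb s_114d3c.mem i) = addr c := h1.symm.trans ((w_kept.get .r14 rfl).trans (c_r14.trans ecw))
      exact addr_inj _ _ (by omega) (by omega) h2
    -- `entries` is the word loaded, non-negative and below 2^24 by K1
    have hk1 := hmid.book.k.k1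
    rw [hc] at hk1
    have een : Codebook.entries v.mem c = sint32 en := by
      simp only [vacc, voff]
      unfold Mem.i32 Mem.u32
      rw [← hen, ecw]
      simp only [vfield]
    have k1a := hk1.ent_nonneg
    have k1b := hk1.ent_lt
    rw [een] at k1a k1b
    have b1 : en < 256 ^ 4 := by
      rw [← hen]
      exact Mem.readLE_lt' v.mem _ 4
    have c1 := sint32_cases en
    have hen' : sint32 en = (en : Int) := by omega
    have hen24 : en < 2 ^ 24 := by omega
    have hle := fix17_le _ en hen24 hbr_114d1e hbr_114d2d
    -- the fields in the final memory
    have hsk : SameK (v.mem.writeLE (g.e.reg Reg.rsp - 1488) 8 1133880) s_114d3c.mem c := by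
      rw [w_mem]
      exact SameK.of_writeLE _ c (c + 28) 4 _ (by omega) (by omega)
    have hR : g.R = (g.e.reg .rsp).toNat - 1480 := rfl
    have hsp : Mem.SameExcept [⟨g.RA - 1488, g.RA - 1480⟩] v.mem (v.mem.writeLE (g.e.reg .rsp - 1488) 8 1133880) := by
      apply Mem.SameExcept.writeLE
      · u_omega
      · refine ⟨_, List.mem_cons_self, ?_, ?_⟩
        · simp only []
          unfold Ghost.RA
          u_omega
        · simp only []
          unfold Ghost.RA
          u_omega
    have hwsp : ∀ w, w ∈ [(⟨g.RA - 1488, g.RA - 1480⟩ : Span)] → OffArena g w := by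
      intro w hw
      have e1 := List.mem_singleton.mp hw
      subst e1
      unfold OffArena Ghost.RA
      simp only []
      omega
    obtain ⟨_, esf⟩ := call_fields hmid hsp hwsp
    rw [hc] at esf
    have e_ent : Codebook.entries s_114d3c.mem c = (en : Int) := by
      have e1 : Codebook.entries s_114d3c.mem c =
          Codebook.entries (v.mem.writeLE (g.e.reg Reg.rsp - 1488) 8 1133880) c := by
        simp only [vacc, voff]
        exact hsk.lo.i32 _ (by omega) (by omega) (by omega)
      rw [e1, esf.entries, een, hen']
    have e_lt : Codebook.lookup_type s_114d3c.mem c = 1 := by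
      have e1 : Codebook.lookup_type s_114d3c.mem c =
          Codebook.lookup_type (v.mem.writeLE (g.e.reg Reg.rsp - 1488) 8 1133880) c := by
        simp only [vacc, voff]
        exact hsk.lt.u8 _ (by omega) (by omega) (by omega)
      rw [e1, esf.lookup_type, ← hc]
      exact hlt1
    have e_lv : Codebook.lookup_values s_114d3c.mem c = (Word.part Width.w32 z).toNat := by
      simp only [vacc, voff]
      unfold Mem.u32
      rw [w_mem, Mem.readLE_writeLE_same _ _ 4 _ (by omega)]
      exact Nat.mod_eq_of_lt (by omega)
    have evb : Codebook.value_bits s_114d3c.mem c = Codebook.value_bits v.mem c := by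
      rw [w_mem, store_keeps_vb _ c (c + 28) 4 _ (by omega) (by omega) (by omega) (by omega)]
      exact esf.value_bits
    refine ReachVia.done (Or.inl ⟨⟨hm, w_rip, ?_⟩, ?_, ?_, ?_⟩)
    · rw [w_kept.get .r15 rfl]
      exact c_r15
    · rw [ec', evb, ← hc]
      exact hvb
    · intro _
      rw [ec', e_lv, e_ent]
      omega
    · intro h2
      rw [ec', e_lt] at h2
      omega

/-- `lea esi, [rax+rax]` on a dword below `2^30`: the double, exactly. -/
theorem dbl32 (lv : Nat) (h : lv < 2 ^ 30) :
    (Word.ofBV (BitVec.setWidth 32 (Word.ofBV (BitVec.ofNat 32 lv) + Word.ofBV (BitVec.ofNat 32 lv)).toBitVec)).toNat % 2 ^ 32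
      = 2 * lv := by
  rw [cnt32_ofBV lv (by omega), Vorbis.toNat_ofBV32]
  simp only [BitVec.toNat_setWidth, UInt64.toNat_toBitVec, UInt64.toNat_add, UInt64.toNat_ofNat']
  omega

/-- **The assertion at the return of `setup_temp_malloc`, `cut156` = 0x114c91**: the common part `Frame`, CUR(i), the book under
construction and `LVFacts` for the arena `A'` after the call, `1 ≤ LV < 2^30`, and the result: NULL (no temp block), or the temp
block `TBlock(rax, 2·LV)`, the only one. -/
structure AtAlloc (u₀ : State) (g : Ghost) (i : Nat) (A2 A3 Ai : Arena) (A' : Arena × List Obj) (s : State) : Prop where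
  fr : Frame u₀ g s.rip A' s
  rip : s.rip = Vorbis.L.start_decoder.cut156
  cur : Cur g i A2 A3 Ai A' s
  book : Book11 g i Ai A' s.mem
  lv : LVFacts s.mem (g.cb s.mem i)
  lv_pos : 1 ≤ Codebook.lookup_values s.mem (g.cb s.mem i)
  lv_lt : Codebook.lookup_values s.mem (g.cb s.mem i) < 2 ^ 30
  res : (s.reg .rax = 0 ∧ A'.1.temps = []) ∨
    ((s.reg .rax).toNat ≠ 0 ∧
      TempsAre A'.1 [((s.reg .rax).toNat, 2 * Codebook.lookup_values s.mem (g.cb s.mem i))])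

/-- **Leg F, 0x114c6f → 0x114c91 ∨ 0x114d58** (C lines 3889 – 3890 up to the return of `setup_temp_malloc`). -/
theorem legF {Lay : Layout} {μ : Microarch} {u₀ : State} (henv : Env0 Lay μ u₀)
    (hld4 : Asan.SmallCheck Lay μ Vorbis.WayInv (Vorbis.CodeOK u₀) [.rax, .rcx, .rdx] 4 Vorbis.L.__asan_load4_noabort.entry)
    (h_stm : ∀ (others : List Obj) (frames : List (Nat × FrameLayout)) (A : Arena),
      Calls Lay μ Vorbis.WayInv (Vorbis.conv u₀) Vorbis.L.setup_temp_malloc.entry (Vorbis.Spec.setup_temp_malloc.spec others frames A))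
    (g : Ghost) (i : Nat) (A2 A3 Ai : Arena) (A : Arena × List Obj) (v : State)
    (hat : AtLV u₀ g i A2 A3 Ai A v) :
    ReachVia Lay μ WayInv v (fun w => (∃ A', AtAlloc u₀ g i A2 A3 Ai A' w) ∨
      (Mid11 u₀ g i A2 A3 Ai A w ∧ w.rip = 0x114d58)) := by
  obtain ⟨hLay, hμ, hcode⟩ := henv
  obtain ⟨⟨hmid, hrip, c_r15⟩, hlvf⟩ := hat
  have he := hmid.fr.entry
  v_entry he
  have w_rip := hrip
  have c_rsp := rsp_form hmid.fr
  have w_eq : Mem.EqOn Vorbis.L.textLo Vorbis.L.textHi u₀.mem v.mem := hmid.fr.code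
  have hdf : v.flags .df = false := (show abiInv _ from hmid.fr.inv).1
  have hmx : v.mxcsr &&& 0x1F80 = 0x1F80 := (show abiInv _ from hmid.fr.inv).2
  have hsse := Vorbis.sseOK_of_abiInv hmid.fr.inv
  have sf : v.mem.readLE (g.e.reg .rsp - 1456) 8 = g.f := by
    have e := slot_form hmid.fr 24 1456 (by omega)
    have hs := hmid.cur.slot_f
    unfold Mem.u64 at hs
    rw [e] at hs
    exact hs
  simp only [depth] at he_room he_stack
  obtain ⟨hw1, hw2, hw3⟩ := obj_where hmid.fr hmid.cur.hand
  unfold Ghost.RA at hw3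
  have hfdef : g.f = (g.e.reg .rdi).toNat := rfl
  have hR : g.R = (g.e.reg .rsp).toNat - 1480 := rfl
  obtain ⟨hc1, hc2, hc3⟩ := cb_where hmid
  obtain ⟨c, hc⟩ : ∃ c, g.cb v.mem i = c := ⟨_, rfl⟩
  rw [hc] at hc1 hc2 hc3
  obtain ⟨cw, c_r14⟩ : ∃ cw, v.reg .r14 = cw := ⟨_, rfl⟩
  have hcw : cw.toNat = c := by
    rw [← c_r14, hmid.cur.r14, hc]
    exact toNat_addr c (by omega)
  have ecw : cw = addr c := eq_addr cw c hcw
  obtain ⟨lv, hlv⟩ : ∃ lv, v.mem.readLE (cw + 28) 4 = lv := ⟨_, rfl⟩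
  have hstm := h_stm A.2 g.frames' A.1
  u_walk hcode [hμ.vendor] until [Vorbis.L.start_decoder.cut156, 0x114d58] span [Vorbis.L.textLo, Vorbis.L.textHi] side (v_side)
  · -- the check of `c->lookup_values`
    have hun : ShadowUntouched v.mem s_114c73.mem := by v_untouched
    refine check_field hmid hun 28 4 (by omega) (by omega) ?_
    rw [hc]
    u_omega
  · v_inv
  · -- pre of setup_temp_malloc(f, 2 * LV)
    obtain ⟨hsh, hb, hun⟩ := call_pre hmid w_mem w_rsp
    have hrdi : (s_114c8c.reg .rdi).toNat = g.f := by
      rw [w_rdi]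
      exact toNat_addr g.f (by omega)
    refine ⟨hsh, ?_, ?_, hmid.cur.hand.arenaText⟩
    · rw [hrdi]
      exact hmid.cur.sd.env.live _ hmid.cur.sd.bits.OB1
    · rw [hrdi]
      apply hmid.cur.sd.arena.frame (by simp only [voff]; omega)
      simp only [voff]
      rw [w_mem]
      exact Mem.eqOn_writeLE v.mem _ 8 _ (g.f + 112) 24 (by u_omega) (by u_omega)
  · -- `lookup_values = 0`: to the error stub
    have hinv : abiInv s_114c7e := by
      refine ⟨?_, ?_⟩
      · rw [w_flags]
        simp only [X86.User.df_setStatus]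
        exact w_df_114c73
      · rw [w_mxcsr]
        exact hmx
    have hm : Mid11 u₀ g i A2 A3 Ai A s_114c7e :=
      hmid.pushed w_mem (w_rsp.trans c_rsp.symm) (w_kept.get .r14 rfl) w_eq hinv
    exact ReachVia.done (Or.inr ⟨hm, w_rip⟩)
  · -- the return of setup_temp_malloc
    v_after_call w_rsp_114c8c w_mem_114c8c
    have c_rdi : s_114c8c.reg .rdi = g.e.reg .rdi := by
      rw [w_rdi_114c8c]
      exact addr_toNat _
    simp only [c_rdi] at w_same
    -- the request is `2 * LV` exactly: `LV < 2^30` (type 1: FIX 17 and K1; type 2: FIX 3)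
    have elv : Codebook.lookup_values v.mem c = lv := by
      simp only [vacc, voff]
      unfold Mem.u32
      rw [← hlv, ecw]
      simp only [vfield]
    have hlv30 : lv < 2 ^ 30 := by
      have hk1 := hmid.book.k.k1
      have hpl := hmid.book.prod_le
      have ht := hmid.book.type_12
      have h1 := hlvf.type1_lv
      have h2 := hlvf.type2_lv
      rw [hc] at hk1 hpl ht h1 h2
      rw [elv] at h1 h2
      have k1b := hk1.ent_lt
      rcases ht with ht | ht
      · have := h1 ht
        omega
      · have := h2 ht
        omega
    have hpos : 1 ≤ lv := by omega
    have hn : (s_114c8c.reg .rsi).toNat % 2 ^ 32 = 2 * lv := by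
      rw [w_rsi_114c8c]
      exact dbl32 lv hlv30
    simp only [hn, Asan.shadowSpan] at w_same
    obtain ⟨hyes, hno⟩ := w_post
    rw [hn] at hyes hno
    have eR : (s_114c8c.reg .rsp).toNat + 8 = g.R := by
      rw [w_rsp_114c8c]
      u_omega
    have hun0 := (call_pre hmid w_mem_114c8c w_rsp_114c8c).2.2
    have hbnd := hmid.cur.sd.arena.bounds
    have htxt := hmid.cur.hand.arenaText
    have etxt : L.textHi = 0x119d40 := rfl
    have hr8 := le_r8 (2 * lv)
    by_cases hfit : A.1.Fits (2 * lv)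
    · -- the request fits: the temp block `mults`
      obtain ⟨hrax, harena, hshadow⟩ := hyes hfit
      rw [eR] at hshadow
      rw [c_rdi] at harena
      unfold Arena.Fits at hfit
      have hs : Mem.SameExcept
          [⟨(g.e.reg .rsp).toNat - 1568, (g.e.reg .rsp).toNat - 1480⟩,
           ⟨(g.e.reg .rdi).toNat + 132, (g.e.reg .rdi).toNat + 136⟩,
           ⟨0xC00000 + (A.1.B + (A.1.T - (r8 (2 * lv) + 32))) / 8,
            0xC00000 + (A.1.B + (A.1.T - (r8 (2 * lv) + 32)) + 2 * lv + 7) / 8⟩] v.mem s_114c8cr.mem := by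
        u_same
      have hws : ∀ w, w ∈ [(⟨(g.e.reg .rsp).toNat - 1568, (g.e.reg .rsp).toNat - 1480⟩ : Span),
           ⟨(g.e.reg .rdi).toNat + 132, (g.e.reg .rdi).toNat + 136⟩,
           ⟨0xC00000 + (A.1.B + (A.1.T - (r8 (2 * lv) + 32))) / 8,
            0xC00000 + (A.1.B + (A.1.T - (r8 (2 * lv) + 32)) + 2 * lv + 7) / 8⟩] → TempSpan g A.1 w := by
        intro w hw
        unfold TempSpan Ghost.RA
        simp only [List.mem_cons, List.mem_nil_iff, or_false] at hw
        rcases hw with rfl | rfl | rfl <;> simp only [] <;> omega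
      obtain ⟨hfr', hcur', hbook', ecb, esf⟩ :=
        alloc_transition hmid (A.1.pushTemp (2 * lv), A.1.newTempObj (2 * lv) :: A.2) (A.1.extends_pushTemp _)
          (fun o ho => List.mem_cons_of_mem _ ho) rfl (by
            intro o ho
            rcases List.mem_cons.mp ho with rfl | ho
            · show L.textHi ≤ A.1.B + _
              omega
            · exact hmid.fr.offText o ho) hs hws harena hshadow (w_rsp.trans c_rsp.symm) (w_kept.get .r14 rfl) w_eq w_inv
      have elv' : Codebook.lookup_values s_114c8cr.mem (g.cb s_114c8cr.mem i) = lv := by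
        rw [ecb, esf.lookup_values, hc, elv]
      refine ReachVia.done (Or.inl ⟨_, hfr', w_rip, hcur', hbook', ?_, ?_, ?_, Or.inr ⟨?_, ?_⟩⟩)
      · rw [ecb]
        refine ⟨?_, ?_, ?_⟩
        · rw [esf.value_bits]
          exact hlvf.vb
        · rw [esf.lookup_type, esf.lookup_values, esf.entries]
          exact hlvf.type1_lv
        · rw [esf.lookup_type, esf.lookup_values, esf.entries, esf.dimensions]
          exact hlvf.type2_lv
      · rw [elv']
        exact hpos
      · rw [elv']
        exact hlv30
      · rw [hrax]
        omega
      · rw [elv']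
        refine ⟨?_, ?_⟩
        · show (A.1.pushTemp (2 * lv)).temps = _
          simp only [Arena.pushTemp, hmid.noTemps, List.map_cons, List.map_nil, hrax]
          rw [Nat.add_sub_cancel_left]
        · intro b hb
          have e1 := List.mem_singleton.mp hb
          subst e1
          show A.1.B ≤ _
          rw [hrax]
          omega
    · -- the request does not fit: NULL, nothing but the callee's frame written
      obtain ⟨hrax, harena, hunp, hfail⟩ := hno hfit
      simp only [w_rsp_114c8c] at hfail
      rw [w_mem_114c8c] at hfail
      clear w_same
      have w_same := hfail
      rw [c_rdi] at harena
      have hs : Mem.SameExcept [⟨(g.e.reg .rsp).toNat - 1568, (g.e.reg .rsp).toNat - 1480⟩] v.mem s_114c8cr.mem := by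
        u_same
      have hws : ∀ w, w ∈ [(⟨(g.e.reg .rsp).toNat - 1568, (g.e.reg .rsp).toNat - 1480⟩ : Span)] → TempSpan g A.1 w := by
        intro w hw
        unfold TempSpan Ghost.RA
        have e1 := List.mem_singleton.mp hw
        subst e1
        simp only []
        omega
      have hun : ShadowUntouched v.mem s_114c8cr.mem := Mem.EqOn.trans hun0 hunp
      obtain ⟨hfr', hcur', hbook', ecb, esf⟩ :=
        alloc_transition hmid A (Arena.Extends.refl _) (fun o ho => ho) rfl hmid.fr.offText hs hws harena
          (hmid.fr.shadow.untouched hun) (w_rsp.trans c_rsp.symm) (w_kept.get .r14 rfl) w_eq w_inv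
      have elv' : Codebook.lookup_values s_114c8cr.mem (g.cb s_114c8cr.mem i) = lv := by
        rw [ecb, esf.lookup_values, hc, elv]
      refine ReachVia.done (Or.inl ⟨_, hfr', w_rip, hcur', hbook', ?_, ?_, ?_, Or.inl ⟨hrax, hmid.noTemps⟩⟩)
      · rw [ecb]
        refine ⟨?_, ?_, ?_⟩
        · rw [esf.value_bits]
          exact hlvf.vb
        · rw [esf.lookup_type, esf.lookup_values, esf.entries]
          exact hlvf.type1_lv
        · rw [esf.lookup_type, esf.lookup_values, esf.entries, esf.dimensions]
          exact hlvf.type2_lv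
      · rw [elv']
        exact hpos
      · rw [elv']
        exact hlv30

/-- **`Frame`, CUR(i), the book under construction over the spill `mov [rsp+28H], rax`** (`trip_transport` for the one store, with or
without a temp block), and the slot read back. -/
theorem spill_transport {u₀ : State} {g : Ghost} {i : Nat} {A2 A3 Ai : Arena} {A : Arena × List Obj} {v s : State}
    (hfr : Frame u₀ g v.rip A v) (hcur : Cur g i A2 A3 Ai A v) (hbook : Book11 g i Ai A v.mem)
    {q m : Nat} (hq : A.1.TBlock q m ∨ (q = 0 ∧ m = 0)) {y : Nat} (hy : y < 2 ^ 64)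
    (hm : s.mem = v.mem.writeLE (g.e.reg .rsp - 1440) 8 y) (hrsp : s.reg .rsp = v.reg .rsp)
    (hr14 : s.reg .r14 = v.reg .r14) (hcode : CodeOK u₀ s.mem) (hinv : abiInv s) :
    Frame u₀ g s.rip A s ∧ Cur g i A2 A3 Ai A s ∧ Book11 g i Ai A s.mem ∧
      g.cb s.mem i = g.cb v.mem i ∧ Codebook.SameFields v.mem s.mem (g.cb v.mem i) ∧ s.mem.u64 (g.R + 0x28) = y := by
  obtain ⟨hra1, hra2, hra3⟩ := hfr.ra
  obtain ⟨hr1, hr2⟩ := hfr.r_eq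
  simp only [depth, steady] at hra2 hr1
  obtain ⟨hw1, hw2, hw3⟩ := obj_where hfr hcur.hand
  have e : (g.e.reg .rsp - 1440).toNat = g.R + 0x28 := by
    unfold Ghost.RA at *
    u_omega
  have hs : Mem.SameExcept [⟨g.R + 0x28, g.R + 0x30⟩] v.mem s.mem := by
    rw [hm]
    apply Mem.SameExcept.writeLE
    · omega
    · refine ⟨_, List.mem_cons_self, ?_, ?_⟩
      · simp only []
        omega
      · simp only []
        omega
  have hws : ∀ w, w ∈ [(⟨g.R + 0x28, g.R + 0x30⟩ : Span)] → LoopSpan g q m w := by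
    intro w hw
    have e1 := List.mem_singleton.mp hw
    subst e1
    exact Or.inr (Or.inl ⟨Nat.le_refl _, Nat.le_refl _⟩)
  have hsh : ShadowUntouched v.mem s.mem := by
    rw [hm]
    exact Mem.eqOn_writeLE v.mem _ 8 y 0xC00000 0x200000 (by omega) (by omega)
  have hb : Bits (g.Blk A) g.len s.mem g.f := by
    rw [hm]
    exact (Reader.store_off_obj hcur.sd.bits _ 8 y (by omega) (by omega)).1.bits
  obtain ⟨h1, h2, h3, h4, h5⟩ := trip_transport hfr hcur hbook hq hs hws hb hsh hrsp hr14 hcode hinv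
  refine ⟨h1, h2, h3, h4, h5, ?_⟩
  have e2 := slot_form hfr 40 1440 (by omega)
  unfold Mem.u64
  rw [e2, hm]
  show (v.mem.writeLE (g.e.reg .rsp - 1440) 8 y).readLE (g.e.reg .rsp - 1440) 8 = y
  rw [Mem.readLE_writeLE_same _ _ 8 _ (by omega)]
  exact Nat.mod_eq_of_lt hy

/-- **Leg G, 0x114c91 → 0x114ca3 ∨ 0x114d6f** (`cut156` → the head of loop 3892 `cut157`, or ERRSTUB(3) of line 3891): the spill of
`mults`, the NULL test, `j = 0` (the literal-0 slot Z24). -/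
theorem legG {Lay : Layout} {μ : Microarch} {u₀ : State} (henv : Env0 Lay μ u₀)
    (g : Ghost) (i : Nat) (A2 A3 Ai : Arena) (A : Arena × List Obj) (v : State)
    (hat : AtAlloc u₀ g i A2 A3 Ai A v) :
    ReachVia Lay μ WayInv v (fun w => (∃ mults, AtHead11 u₀ g i A2 A3 Ai A mults 0 w) ∨
      (Mid11 u₀ g i A2 A3 Ai A w ∧ w.rip = 0x114d6f)) := by
  obtain ⟨hLay, hμ, hcode⟩ := henv
  obtain ⟨hfr, hrip, hcur, hbook, hlvf, hlvpos, hlvlt, hres⟩ := hat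
  have he := hfr.entry
  v_entry he
  have w_rip := hrip
  have c_rsp := rsp_form hfr
  have w_eq : Mem.EqOn Vorbis.L.textLo Vorbis.L.textHi u₀.mem v.mem := hfr.code
  have hdf : v.flags .df = false := (show abiInv _ from hfr.inv).1
  have hmx : v.mxcsr &&& 0x1F80 = 0x1F80 := (show abiInv _ from hfr.inv).2
  have hsse := Vorbis.sseOK_of_abiInv hfr.inv
  have sz : v.mem.readLE (g.e.reg .rsp - 1444) 4 = 0 := by
    have e := slot_form hfr 36 1444 (by omega)
    have hs := hcur.sd.frame.z24 (by decide) (by decide)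
    unfold Mem.u32 at hs
    rw [e] at hs
    exact hs
  simp only [depth] at he_room he_stack
  obtain ⟨hw1, hw2, hw3⟩ := obj_where hfr hcur.hand
  unfold Ghost.RA at hw3
  have hR : g.R = (g.e.reg .rsp).toNat - 1480 := rfl
  obtain ⟨p, c_rax⟩ : ∃ p, v.reg .rax = p := ⟨_, rfl⟩
  rw [c_rax] at hres
  u_walk hcode [hμ.vendor] until [Vorbis.L.start_decoder.cut157, 0x114d6f] span [Vorbis.L.textLo, Vorbis.L.textHi] side (v_side)
  · -- `mults == NULL`: to ERRSTUB(3)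
    have hnt : A.1.temps = [] := by
      rcases hres with h | h
      · exact h.2
      · exact absurd hbr_114c99 h.1
    have hinv : abiInv s_114c99 := by
      refine ⟨?_, ?_⟩
      · rw [w_flags]
        simp only [X86.User.df_setStatus]
        exact hdf
      · rw [w_mxcsr]
        exact hmx
    obtain ⟨h1, h2, h3, _, _, _⟩ := spill_transport (s := s_114c99) hfr hcur hbook (Or.inr ⟨rfl, rfl⟩) (UInt64.toNat_lt p)
      w_mem (w_kept.get .rsp rfl) (w_kept.get .r14 rfl) w_eq hinv
    exact ReachVia.done (Or.inr ⟨⟨h1, h2, h3, hnt⟩, w_rip⟩)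
  · -- the temp block is there: `j = 0`, the loop head
    have htemps := (hres.resolve_left (fun h => hbr_114c99 (by rw [h.1]; rfl))).2
    have hinv : abiInv s_114c9f := by
      refine ⟨?_, ?_⟩
      · rw [w_flags]
        simp only [X86.User.df_setStatus]
        exact hdf
      · rw [w_mxcsr]
        exact hmx
    obtain ⟨h1, h2, h3, ecb, esf, hslot⟩ := spill_transport (s := s_114c9f) hfr hcur hbook
      (Or.inl (htemps.tblock List.mem_cons_self)) (UInt64.toNat_lt p)
      w_mem (w_kept.get .rsp rfl) (w_kept.get .r14 rfl) w_eq hinv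
    have elv : Codebook.lookup_values s_114c9f.mem (g.cb s_114c9f.mem i) = Codebook.lookup_values v.mem (g.cb v.mem i) := by
      rw [ecb, esf.lookup_values]
    refine ReachVia.done (Or.inl ⟨p.toNat, h1, w_rip, h2, h3, ⟨hslot, ?_, ?_, ?_⟩, ?_, ?_, ?_⟩)
    · rw [elv]
      exact htemps
    · rw [elv]
      exact hlvpos
    · rw [elv]
      exact hlvlt
    · rw [ecb]
      refine ⟨?_, ?_, ?_⟩
      · rw [esf.value_bits]
        exact hlvf.vb
      · rw [esf.lookup_type, esf.lookup_values, esf.entries]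
        exact hlvf.type1_lv
      · rw [esf.lookup_type, esf.lookup_values, esf.entries, esf.dimensions]
        exact hlvf.type2_lv
    · rw [w_rbp]
      rfl
    · exact Nat.zero_le _

/-- **What every state of loop 3892 satisfies** (`AtHead11` without the program counter and the counter): the common part `Frame` at
the state's own `rip`, CUR(i), the book under construction, the temp block `mults` with its spill slot, `LVFacts`. -/
structure Trip (u₀ : State) (g : Ghost) (i : Nat) (A2 A3 Ai : Arena) (A : Arena × List Obj) (mults : Nat) (s : State) : Prop where
  fr : Frame u₀ g s.rip A s
  cur : Cur g i A2 A3 Ai A s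
  book : Book11 g i Ai A s.mem
  mults : Mults g A s.mem (g.cb s.mem i) mults
  lv : LVFacts s.mem (g.cb s.mem i)

/-- The loop-head assertion gives the record. -/
theorem AtHead11.trip {u₀ : State} {g : Ghost} {i : Nat} {A2 A3 Ai : Arena} {A : Arena × List Obj} {mults j : Nat} {s : State}
    (h : AtHead11 u₀ g i A2 A3 Ai A mults j s) : Trip u₀ g i A2 A3 Ai A mults s :=
  ⟨h.fr, h.cur, h.book, h.mults, h.lv⟩

/-- A span the loop may write besides the spill slot: `OffArena` (the stack below `R`, the reader windows of `*f`) or a range inside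
the temp block `⟨q, m⟩`. -/
def TripSpan (g : Ghost) (q m : Nat) (w : Span) : Prop :=
  OffArena g w ∨ (q ≤ w.lo ∧ w.hi ≤ q + m)

/-- **`Trip` over a footprint of `TripSpan`s** (a check call's pushed return address, `get_bits`, `mults[j] = q`): `trip_transport`
plus the spill slot of `mults`, which no such span meets, and the fields `LVFacts` / `Mults` read. -/
theorem Trip.transport {u₀ : State} {g : Ghost} {i : Nat} {A2 A3 Ai : Arena} {A : Arena × List Obj} {mults : Nat} {v s : State}
    (h : Trip u₀ g i A2 A3 Ai A mults v) {ws : List Span} (hs : Mem.SameExcept ws v.mem s.mem)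
    (hws : ∀ w, w ∈ ws → TripSpan g mults (2 * Codebook.lookup_values v.mem (g.cb v.mem i)) w)
    (hb : Bits (g.Blk A) g.len s.mem g.f) (hsh : ShadowUntouched v.mem s.mem) (hrsp : s.reg .rsp = v.reg .rsp)
    (hr14 : s.reg .r14 = v.reg .r14) (hcode : CodeOK u₀ s.mem) (hinv : abiInv s) :
    Trip u₀ g i A2 A3 Ai A mults s ∧ g.cb s.mem i = g.cb v.mem i ∧
      Codebook.SameFields v.mem s.mem (g.cb v.mem i) := by
  obtain ⟨hfr, hcur, hbook, hmu, hlvf⟩ := h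
  have hq : A.1.TBlock mults (2 * Codebook.lookup_values v.mem (g.cb v.mem i)) := hmu.temps.tblock List.mem_cons_self
  have hws' : ∀ w, w ∈ ws → LoopSpan g mults (2 * Codebook.lookup_values v.mem (g.cb v.mem i)) w := by
    intro w hw
    rcases hws w hw with h0 | h0
    · exact Or.inl h0
    · exact Or.inr (Or.inr h0)
  obtain ⟨h1, h2, h3, ecb, esf⟩ := trip_transport hfr hcur hbook (Or.inl hq) hs hws' hb hsh hrsp hr14 hcode hinv
  -- the spill slot of `mults`
  obtain ⟨hw1, hw2, hw3⟩ := obj_where hfr hcur.hand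
  obtain ⟨hra1, hra2, hra3⟩ := hfr.ra
  obtain ⟨hr1, hr2⟩ := hfr.r_eq
  simp only [depth, steady] at hra2 hr1
  have ha := hcur.sd.arena
  have hbnd := ha.bounds
  have htr := ha.tblock_range hq
  have hto := ha.tblock_off hq
  have eslot : Mem.EqOn (g.R + 0x28) (g.R + 0x30) v.mem s.mem := by
    apply hs.eqOn
    intro w hw
    have := hws w hw
    unfold TripSpan OffArena at this
    omega
  have elv : Codebook.lookup_values s.mem (g.cb s.mem i) = Codebook.lookup_values v.mem (g.cb v.mem i) := by
    rw [ecb, esf.lookup_values]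
  refine ⟨⟨h1, h2, h3, ⟨?_, ?_, ?_, ?_⟩, ?_⟩, ecb, esf⟩
  · exact (eslot.u64 (g.R + 0x28) (by omega) (by omega) (by omega)).trans hmu.slot
  · rw [elv]
    exact hmu.temps
  · rw [elv]
    exact hmu.lv_pos
  · rw [elv]
    exact hmu.lv_lt
  · rw [ecb]
    refine ⟨?_, ?_, ?_⟩
    · rw [esf.value_bits]
      exact hlvf.vb
    · rw [esf.lookup_type, esf.lookup_values, esf.entries]
      exact hlvf.type1_lv
    · rw [esf.lookup_type, esf.lookup_values, esf.entries, esf.dimensions]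
      exact hlvf.type2_lv

/-- `call_pre` for a state of the loop (`Trip` instead of `Mid11`). -/
theorem Trip.call_pre {u₀ : State} {g : Ghost} {i : Nat} {A2 A3 Ai : Arena} {A : Arena × List Obj} {mults : Nat} {v s : State}
    (h : Trip u₀ g i A2 A3 Ai A mults v) {x : Nat} (hm : s.mem = v.mem.writeLE (g.e.reg .rsp - 1488) 8 x)
    (hrsp : s.reg .rsp = g.e.reg .rsp - 1488) :
    ShadowPre A.2 g.frames' s ∧ Bits (g.Blk A) g.len s.mem g.f ∧ ShadowUntouched v.mem s.mem := by
  obtain ⟨hw1, hw2, hw3⟩ := obj_where h.fr h.cur.hand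
  obtain ⟨hra1, hra2, hra3⟩ := h.fr.ra
  obtain ⟨hr1, hr2⟩ := h.fr.r_eq
  simp only [depth, steady] at hra2 hr1
  unfold Ghost.RA at hra1 hra2 hra3 hr1 hw3
  have e : (g.e.reg .rsp - 1488).toNat = (g.e.reg .rsp).toNat - 1488 := by u_omega
  have hun : ShadowUntouched v.mem s.mem := by
    rw [hm]
    exact Mem.eqOn_writeLE v.mem _ 8 x 0xC00000 0x200000 (by omega) (by omega)
  refine ⟨shadowPre_call h.fr ?_ hun, ?_, hun⟩
  · rw [hrsp, e]
    omega
  · rw [hm]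
    exact (Reader.store_off_obj h.cur.sd.bits _ 8 x (by omega) (by omega)).1.bits

/-- `check_field` for a state of the loop. -/
theorem Trip.check_field {u₀ : State} {g : Ghost} {i : Nat} {A2 A3 Ai : Arena} {A : Arena × List Obj} {mults : Nat} {v : State}
    {mem' : Mem} (h : Trip u₀ g i A2 A3 Ai A mults v) (hun : ShadowUntouched v.mem mem') (off n : Nat)
    (hoff : off + n ≤ 2120) (hn : 1 ≤ n) {b : Word} (hb : b.toNat = g.cb v.mem i + off) : AccSmall n mem' b := by
  have hok := (h.cur.sd.cb0 (by omega)).1.ok (h.cur.sd.cb0 (by omega)).2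
  have hs := hok.site_cb_field h.cur.sd.env.live i h.cur.lt off n (by simp only [voff]; omega) hn rfl
  exact check_site h.fr.shadow hun hs hb

/-- `cb_where` for a state of the loop. -/
theorem Trip.cb_where {u₀ : State} {g : Ghost} {i : Nat} {A2 A3 Ai : Arena} {A : Arena × List Obj} {mults : Nat} {v : State}
    (h : Trip u₀ g i A2 A3 Ai A mults v) :
    0x119d40 ≤ g.cb v.mem i ∧ g.cb v.mem i + 2120 ≤ 0xC00000 ∧
      (g.cb v.mem i + 2120 ≤ 0x700000 ∨ 0x800000 ≤ g.cb v.mem i) := by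
  have ha := h.cur.sd.arena
  have hcb := h.cur.ages.cbOK
  have hcbA : A.1.Blk (codebooksBlock v.mem g.f) := hcb.F2.mono h.cur.ages.exti
  have hci := hcb.cb_in i h.cur.lt
  have hstk := ha.blk_off_stack hcbA
  have hins := arena_inside ha hcbA
  have hbnd := ha.bounds
  have htxt := h.cur.hand.arenaText
  have etxt : L.textHi = 0x119d40 := rfl
  have hc : g.cb v.mem i = stb_vorbis.codebooks_at v.mem g.f i := rfl
  simp only [vblock, voff] at hci hstk hins
  omega

/-- **`Trip` over a word pushed at `[R − 8]`** (the return address of a check call) at a state with that memory. -/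
theorem Trip.pushed {u₀ : State} {g : Ghost} {i : Nat} {A2 A3 Ai : Arena} {A : Arena × List Obj} {mults : Nat} {v s : State}
    (h : Trip u₀ g i A2 A3 Ai A mults v) {y : Nat} (hm : s.mem = v.mem.writeLE (g.e.reg .rsp - 1488) 8 y)
    (hrsp : s.reg .rsp = v.reg .rsp) (hr14 : s.reg .r14 = v.reg .r14) (hcode : CodeOK u₀ s.mem) (hinv : abiInv s) :
    Trip u₀ g i A2 A3 Ai A mults s ∧ g.cb s.mem i = g.cb v.mem i ∧
      Codebook.SameFields v.mem s.mem (g.cb v.mem i) := by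
  obtain ⟨hra1, hra2, hra3⟩ := h.fr.ra
  obtain ⟨hr1, hr2⟩ := h.fr.r_eq
  simp only [depth, steady] at hra2 hr1
  obtain ⟨hw1, hw2, hw3⟩ := obj_where h.fr h.cur.hand
  have e : (g.e.reg .rsp - 1488).toNat = g.RA - 1488 := by
    unfold Ghost.RA at *
    u_omega
  have hs : Mem.SameExcept [⟨g.RA - 1488, g.RA - 1480⟩] v.mem s.mem := by
    rw [hm]
    apply Mem.SameExcept.writeLE
    · omega
    · refine ⟨_, List.mem_cons_self, ?_, ?_⟩
      · simp only []
        omega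
      · simp only []
        omega
  have hws : ∀ w, w ∈ [(⟨g.RA - 1488, g.RA - 1480⟩ : Span)] →
      TripSpan g mults (2 * Codebook.lookup_values v.mem (g.cb v.mem i)) w := by
    intro w hw
    have e1 := List.mem_singleton.mp hw
    subst e1
    left
    unfold OffArena
    simp only []
    omega
  have hsh : ShadowUntouched v.mem s.mem := by
    rw [hm]
    exact Mem.eqOn_writeLE v.mem _ 8 y 0xC00000 0x200000 (by omega) (by omega)
  have hb : Bits (g.Blk A) g.len s.mem g.f := by
    rw [hm]
    exact (Reader.store_off_obj h.cur.sd.bits _ 8 y (by omega) (by omega)).1.bits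
  exact h.transport hs hws hb hsh hrsp hr14 hcode hinv

/-- With `rip` at `cut165` and `rbx = LV` the loop's record IS `InC12`. -/
theorem Trip.toInC12 {u₀ : State} {g : Ghost} {i : Nat} {A2 A3 Ai : Arena} {A : Arena × List Obj} {mults : Nat} {s : State}
    (h : Trip u₀ g i A2 A3 Ai A mults s) (hfr : Frame u₀ g pc_C12 A s)
    (hrbx : s.reg .rbx = addr (Codebook.lookup_values s.mem (g.cb s.mem i))) : InC12 u₀ g i A2 A3 Ai A mults s :=
  { frame := hfr
    cur := h.cur
    k := h.book.k
    type_12 := h.book.type_12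
    prod_le := h.book.prod_le
    rbx := hrbx
    mults := h.mults
    type1_lv := h.lv.type1_lv
    type2_lv := h.lv.type2_lv
    vb := h.lv.vb
    mu0 := h.book.mu0 }

/-- `movzx esi, byte [m]`: the byte. -/
theorem zx8 (b : Nat) (h : b < 256) : (Word.ofBV (BitVec.zeroExtend 32 (BitVec.ofNat 8 b))).toNat = b := by
  rw [Vorbis.toNat_ofBV32]
  simp only [BitVec.truncate_eq_setWidth, BitVec.toNat_setWidth, BitVec.toNat_ofNat]
  omega

/-- **The assertion at the return of the loop's `get_bits`, `cut158` = 0x114cd0**: `Trip`, ebp = j < LV, the result below `2^16`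
(`value_bits ≤ 16`): it is never `EOP = −1`. -/
structure AtBody11 (u₀ : State) (g : Ghost) (i : Nat) (A2 A3 Ai : Arena) (A : Arena × List Obj) (mults j : Nat) (s : State) :
    Prop where
  trip : Trip u₀ g i A2 A3 Ai A mults s
  rip : s.rip = Vorbis.L.start_decoder.cut158
  rbp : s.reg .rbp = addr j
  j_lt : j < Codebook.lookup_values s.mem (g.cb s.mem i)
  rax : (s.reg .rax).toNat < 2 ^ 16

/-- **Leg H1, the head of loop 3892, 0x114ca3 → 0x114db9 (exit: `AtC12`) ∨ 0x114cd0** (`cut157` → `cut165` or `cut158`): the loop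
test `j < (int) c->lookup_values`, then `get_bits(f, c->value_bits)`. -/
theorem legH1 {Lay : Layout} {μ : Microarch} {u₀ : State} (henv : Env0 Lay μ u₀)
    (hld4 : Asan.SmallCheck Lay μ Vorbis.WayInv (Vorbis.CodeOK u₀) [.rax, .rcx, .rdx] 4 Vorbis.L.__asan_load4_noabort.entry)
    (hld1 : Asan.SmallCheck Lay μ Vorbis.WayInv (Vorbis.CodeOK u₀) [.rax, .rdx] 1 Vorbis.L.__asan_load1_noabort.entry)
    (h_get_bits : ∀ (others : List Obj) (frames : List (Nat × FrameLayout)) (Blk : Block → Prop) (len : Nat),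
      Calls Lay μ Vorbis.WayInv (Vorbis.conv u₀) Vorbis.L.get_bits.entry (Vorbis.Spec.get_bits.spec others frames Blk len))
    (g : Ghost) (i : Nat) (A2 A3 Ai : Arena) (A : Arena × List Obj) (mults j : Nat) (v : State)
    (hat : AtHead11 u₀ g i A2 A3 Ai A mults j v) :
    ReachVia Lay μ WayInv v (fun w => AtC12 u₀ g i w ∨ AtBody11 u₀ g i A2 A3 Ai A mults j w) := by
  obtain ⟨hLay, hμ, hcode⟩ := henv
  have htrip := hat.trip
  obtain ⟨hfr, hrip, hcur, hbook, hmu, hlvf, hrbp, hjle⟩ := hat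
  have he := hfr.entry
  v_entry he
  have w_rip := hrip
  have c_rsp := rsp_form hfr
  have w_eq : Mem.EqOn Vorbis.L.textLo Vorbis.L.textHi u₀.mem v.mem := hfr.code
  have hdf : v.flags .df = false := (show abiInv _ from hfr.inv).1
  have hmx : v.mxcsr &&& 0x1F80 = 0x1F80 := (show abiInv _ from hfr.inv).2
  have hsse := Vorbis.sseOK_of_abiInv hfr.inv
  have sf : v.mem.readLE (g.e.reg .rsp - 1456) 8 = g.f := by
    have e := slot_form hfr 24 1456 (by omega)
    have hs := hcur.slot_f
    unfold Mem.u64 at hs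
    rw [e] at hs
    exact hs
  have hgb := h_get_bits A.2 g.frames' (g.Blk A) g.len
  simp only [depth] at he_room he_stack
  obtain ⟨hw1, hw2, hw3⟩ := obj_where hfr hcur.hand
  unfold Ghost.RA at hw3
  have hfdef : g.f = (g.e.reg .rdi).toNat := rfl
  have hR : g.R = (g.e.reg .rsp).toNat - 1480 := rfl
  obtain ⟨hc1, hc2, hc3⟩ := htrip.cb_where
  obtain ⟨c, hc⟩ : ∃ c, g.cb v.mem i = c := ⟨_, rfl⟩
  rw [hc] at hc1 hc2 hc3
  obtain ⟨cw, c_r14⟩ : ∃ cw, v.reg .r14 = cw := ⟨_, rfl⟩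
  have hcw : cw.toNat = c := by
    rw [← c_r14, hcur.r14, hc]
    exact toNat_addr c (by omega)
  have ecw : cw = addr c := eq_addr cw c hcw
  obtain ⟨lv, hlv⟩ : ∃ lv, v.mem.readLE (cw + 28) 4 = lv := ⟨_, rfl⟩
  obtain ⟨vb, hvb⟩ : ∃ vb, v.mem.readLE (cw + 24) 1 = vb := ⟨_, rfl⟩
  have elv : Codebook.lookup_values v.mem c = lv := by
    simp only [vacc, voff]
    unfold Mem.u32
    rw [← hlv, ecw]
    simp only [vfield]
  have evb : Codebook.value_bits v.mem c = vb := by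
    simp only [vacc, voff]
    unfold Mem.u8
    rw [← hvb, ecw]
    simp only [vfield]
  have hlv30 := hmu.lv_lt
  have hvb16 := hlvf.vb
  rw [hc] at hlv30 hvb16 hjle
  rw [elv] at hlv30 hjle
  rw [evb] at hvb16
  have c_rbp : v.reg .rbp = UInt64.ofNat j := hrbp
  u_walk hcode [hμ.vendor, cnt32_part j] until [Vorbis.L.start_decoder.cut165, Vorbis.L.start_decoder.cut158]
    span [Vorbis.L.textLo, Vorbis.L.textHi] side (v_side)
  · -- the check of `c->lookup_values`
    have hun : ShadowUntouched v.mem s_114ca7.mem := by v_untouched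
    refine htrip.check_field hun 28 4 (by omega) (by omega) ?_
    rw [hc]
    u_omega
  · -- the check of `c->value_bits`
    have hun : ShadowUntouched v.mem s_114cbc.mem := by v_untouched
    refine htrip.check_field hun 24 1 (by omega) (by omega) ?_
    rw [hc]
    u_omega
  · v_inv
  · -- pre of get_bits(f, value_bits)
    obtain ⟨hsh, hb, hun⟩ := htrip.call_pre w_mem w_rsp
    have hrdi : (s_114ccb.reg .rdi).toNat = g.f := by
      rw [w_rdi]
      exact toNat_addr g.f (by omega)
    refine ⟨⟨hsh, ?_, ?_⟩, ?_⟩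
    · rw [hrdi]
      exact readerEnv hcur.hand hcur.sd.env.live
    · rw [hrdi]
      exact hb
    · rw [bitsArg_def, w_rsi, zx8 vb (by omega)]
      omega
  · -- `LV ≤ j`: the exit of the loop, `AtC12`
    unfold addr at hbr_114cb2
    rw [cnt32_part_toInt j (by omega), cnt32_toInt lv (by omega)] at hbr_114cb2
    have hinv : abiInv s_114cb2 := by
      refine ⟨?_, ?_⟩
      · rw [w_flags]
        simp only [X86.User.df_setStatus]
        exact w_df_114ca7
      · rw [w_mxcsr]
        exact hmx
    obtain ⟨ht', ecb, esf⟩ := htrip.pushed w_mem (w_rsp.trans c_rsp.symm) (w_kept.get .r14 rfl) w_eq hinv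
    have hfr' : Frame u₀ g pc_C12 A s_114cb2 := by
      have := ht'.fr
      rw [w_rip] at this
      exact this
    refine ReachVia.done (Or.inl ⟨A, mults, A2, A3, Ai, ht'.toInC12 hfr' ?_⟩)
    rw [w_rbx, cnt32_ofBV lv (by omega), ecb, esf.lookup_values, hc, elv]
    rfl
  · -- the return of get_bits: the result is below `2^16`
    unfold addr at hbr_114cb2
    rw [cnt32_part_toInt j (by omega), cnt32_toInt lv (by omega)] at hbr_114cb2
    v_after_call w_rsp_114ccb w_mem_114ccb
    have c_rdi : s_114ccb.reg .rdi = g.e.reg .rdi := by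
      rw [w_rdi_114ccb]
      exact addr_toNat _
    simp only [c_rdi] at w_same
    obtain ⟨_, _, hun0⟩ := htrip.call_pre w_mem_114ccb w_rsp_114ccb
    have hun : ShadowUntouched v.mem s_114ccbr.mem := Mem.EqOn.trans hun0 w_post.untouched
    have hsame : Mem.SameExcept
        [⟨(g.e.reg .rsp).toNat - 1840, (g.e.reg .rsp).toNat - 1480⟩,
         ⟨(g.e.reg .rdi).toNat + 48, (g.e.reg .rdi).toNat + 56⟩, ⟨(g.e.reg .rdi).toNat + 84, (g.e.reg .rdi).toNat + 96⟩,
         ⟨(g.e.reg .rdi).toNat + 136, (g.e.reg .rdi).toNat + 144⟩, ⟨(g.e.reg .rdi).toNat + 1484, (g.e.reg .rdi).toNat + 1749⟩,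
         ⟨(g.e.reg .rdi).toNat + 1752, (g.e.reg .rdi).toNat + 1784⟩] v.mem s_114ccbr.mem := by
      u_same
    have hb1 : Bits (g.Blk A) g.len s_114ccbr.mem g.f := by
      have hb := w_post.bits.bits
      rw [c_rdi] at hb
      exact hb
    obtain ⟨ht', ecb, esf⟩ := htrip.transport hsame (by
      intro w hw
      left
      unfold OffArena Ghost.RA
      simp only [List.mem_cons, List.mem_nil_iff, or_false] at hw
      rcases hw with rfl | rfl | rfl | rfl | rfl | rfl <;> simp only [] <;> omega)
      hb1 hun (w_rsp.trans c_rsp.symm) (w_kept.get .r14 rfl) w_eq w_inv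
    have hres := w_post.bits.result
    have harg : bitsArg s_114ccb = vb := by
      rw [bitsArg_def, w_rsi_114ccb, zx8 vb (by omega)]
      omega
    rw [harg] at hres
    have hz := hres.2 (by omega)
    have hp : 2 ^ vb ≤ 2 ^ 16 := Nat.pow_le_pow_right (by omega) hvb16.2
    refine ReachVia.done (Or.inr ⟨ht', w_rip, ?_, ?_, ?_⟩)
    · rw [w_kept.get .rbp rfl]
      exact hrbp
    · rw [ecb, esf.lookup_values, hc, elv]
      omega
    · omega

/-- **Leg H2, the body of loop 3892 after `get_bits`, 0x114cd0 → 0x114ca3** (`cut158` → the head `cut157` with `j + 1`): the `EOP`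
test (dead: the result is below `2^16`), the check of `mults[j]`, the store, `++j`. -/
theorem legH2 {Lay : Layout} {μ : Microarch} {u₀ : State} (henv : Env0 Lay μ u₀)
    (hst2 : Asan.SmallCheck Lay μ Vorbis.WayInv (Vorbis.CodeOK u₀) [.rax, .rcx, .rdx] 2 Vorbis.L.__asan_store2_noabort.entry)
    (g : Ghost) (i : Nat) (A2 A3 Ai : Arena) (A : Arena × List Obj) (mults j : Nat) (v : State)
    (hat : AtBody11 u₀ g i A2 A3 Ai A mults j v) :
    ReachVia Lay μ WayInv v (fun w => AtHead11 u₀ g i A2 A3 Ai A mults (j + 1) w) := by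
  obtain ⟨hLay, hμ, hcode⟩ := henv
  obtain ⟨htrip, hrip, hrbp, hjlt, hrax⟩ := hat
  have hfr := htrip.fr
  have hcur := htrip.cur
  have hmu := htrip.mults
  have he := hfr.entry
  v_entry he
  have w_rip := hrip
  have c_rsp := rsp_form hfr
  have w_eq : Mem.EqOn Vorbis.L.textLo Vorbis.L.textHi u₀.mem v.mem := hfr.code
  have hdf : v.flags .df = false := (show abiInv _ from hfr.inv).1
  have hmx : v.mxcsr &&& 0x1F80 = 0x1F80 := (show abiInv _ from hfr.inv).2
  have hsse := Vorbis.sseOK_of_abiInv hfr.inv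
  have sm : v.mem.readLE (g.e.reg .rsp - 1440) 8 = mults := by
    have e := slot_form hfr 40 1440 (by omega)
    have hs := hmu.slot
    unfold Mem.u64 at hs
    rw [e] at hs
    exact hs
  simp only [depth] at he_room he_stack
  obtain ⟨hw1, hw2, hw3⟩ := obj_where hfr hcur.hand
  unfold Ghost.RA at hw3
  have hR : g.R = (g.e.reg .rsp).toNat - 1480 := rfl
  have hq : A.1.TBlock mults (2 * Codebook.lookup_values v.mem (g.cb v.mem i)) := hmu.temps.tblock List.mem_cons_self
  have hto := hcur.sd.arena.tblock_off hq
  have htr := hcur.sd.arena.tblock_range hq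
  have hout := hcur.objOut
  simp only [Off.sizeof.stb_vorbis] at hout
  have hbnd := hcur.sd.arena.bounds
  have hlv30 := hmu.lv_lt
  obtain ⟨lv, elv⟩ : ∃ lv, Codebook.lookup_values v.mem (g.cb v.mem i) = lv := ⟨_, rfl⟩
  rw [elv] at hq hto htr hlv30 hjlt
  have hr8 := le_r8 (2 * lv)
  have htxt := hcur.hand.arenaText
  have etxt : L.textHi = 0x119d40 := rfl
  have c_rbp : v.reg .rbp = UInt64.ofNat j := hrbp
  clear hrbp
  obtain ⟨z, c_rax⟩ : ∃ z, v.reg .rax = z := ⟨_, rfl⟩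
  rw [c_rax] at hrax
  have hj31 : j < 2 ^ 31 := by omega
  u_walk hcode [hμ.vendor, cnt32_part j, cnt32_sext_bv j hj31] until [Vorbis.L.start_decoder.cut157, 0x114d86]
    span [Vorbis.L.textLo, Vorbis.L.textHi] side (v_side)
  · -- the check of `mults[j]`: inside the temp block
    have ea : (UInt64.ofNat j + UInt64.ofNat j + UInt64.ofNat mults).toNat = mults + 2 * j := by u_omega
    have hun : ShadowUntouched v.mem s_114ced.mem := by v_untouched
    have hlive := hcur.sd.arena.tblock_live_inv hfr.shadow hq
    exact check_site hfr.shadow hun (Site.of_block hlive (by show mults ≤ _; omega) (by show _ ≤ mults + 2 * lv; omega)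
      (by omega)) ea
  · -- the store misses the text
    have ea : (UInt64.ofNat j + UInt64.ofNat j + UInt64.ofNat mults).toNat = mults + 2 * j := by u_omega
    rw [ea]
    omega
  · -- `q == EOP` is impossible: the result of `get_bits(f, value_bits)` is below `2^16`
    exfalso
    rw [Vorbis.toNat_part32] at hbr_114cd6
    simp only [Width.bits] at hbr_114cd6
    omega
  · -- the store `mults[j] = q`, `++j`, back to the head
    have ea : (UInt64.ofNat j + UInt64.ofNat j + UInt64.ofNat mults).toNat = mults + 2 * j := by u_omega
    have hsame : Mem.SameExcept
        [⟨(g.e.reg .rsp).toNat - 1488, (g.e.reg .rsp).toNat - 1480⟩, ⟨mults + 2 * j, mults + 2 * j + 2⟩]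
        v.mem s_114cf9.mem := by
      rw [w_mem]
      apply Mem.SameExcept.step_writeLE
      · apply Mem.SameExcept.writeLE
        · u_omega
        · refine ⟨_, List.mem_cons_self, ?_, ?_⟩
          · simp only []
            u_omega
          · simp only []
            u_omega
      · rw [ea]
        omega
      · refine ⟨_, List.mem_cons_of_mem _ List.mem_cons_self, ?_, ?_⟩
        · simp only []
          omega
        · simp only []
          omega
    have hws : ∀ w, w ∈ [(⟨(g.e.reg .rsp).toNat - 1488, (g.e.reg .rsp).toNat - 1480⟩ : Span),
        ⟨mults + 2 * j, mults + 2 * j + 2⟩] →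
        TripSpan g mults (2 * Codebook.lookup_values v.mem (g.cb v.mem i)) w := by
      intro w hw
      rw [elv]
      unfold TripSpan OffArena Ghost.RA
      simp only [List.mem_cons, List.mem_nil_iff, or_false] at hw
      rcases hw with rfl | rfl <;> simp only [] <;> omega
    have hun : ShadowUntouched v.mem s_114cf9.mem := by v_untouched
    have hb : Bits (g.Blk A) g.len s_114cf9.mem g.f := by
      apply bits_off hcur.sd.bits hsame
      intro w hw
      simp only [List.mem_cons, List.mem_nil_iff, or_false] at hw
      rcases hw with rfl | rfl <;> simp only [] <;> omega
    have hinv : abiInv s_114cf9 := by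
      refine ⟨?_, ?_⟩
      · rw [w_flags]
        simp only [X86.User.df_setStatus]
        exact w_df_114ced
      · rw [w_mxcsr]
        exact hmx
    obtain ⟨ht', ecb, esf⟩ :=
      htrip.transport hsame hws hb hun (w_rsp.trans c_rsp.symm) (w_kept.get .r14 rfl) w_eq hinv
    refine ReachVia.done ⟨ht'.fr, w_rip, ht'.cur, ht'.book, ht'.mults, ht'.lv, ?_, ?_⟩
    · rw [w_rbp, ← cnt32_part j, cnt32_succ j (by omega)]
      rfl
    · rw [ecb, esf.lookup_values, elv]
      omega

end Vorbis.Spec.start_decoder_C11
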